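-- pv_equiv track=rewrite | github.com/Andreasdahlberg/advent-of-code-2018 | day 14/chocolate.py | get_part_two_answer
-- ===== SOURCE A (Python) =====
-- def get_part_two_answer(puzzle_input):
--     scoreboard = [3, 7]
--     current_recipes = [0, 1]
--
--     sequence = str(puzzle_input)
--     current_sequence = ''.join([str(c) for c in scoreboard])
--     counter = len(scoreboard)
--
--     while True:
--         score_sum = get_new_recipe_sum(scoreboard, current_recipes)
--         for c in str(score_sum):
--             scoreboard.append(int(c))
--             counter += 1
--
--             if len(current_sequence) == len(sequence):
--                 current_sequence = current_sequence[1:] + c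
--             else:
--                 current_sequence = current_sequence + c
--
--             if current_sequence == sequence:
--                 return counter - len(sequence)
--
--         current_recipes[0] = (current_recipes[0] + scoreboard[current_recipes[0]] + 1) % len(scoreboard)
--         current_recipes[1] = (current_recipes[1] + scoreboard[current_recipes[1]] + 1) % len(scoreboard)
--
-- def get_new_recipe_sum(scoreboard, current_recipes):
--     return scoreboard[current_recipes[0]] + scoreboard[current_recipes[1]]
-- ===== SOURCE B (Python) =====
-- def get_part_two_answer(puzzle_input):
--     target = str(puzzle_input)
--     n = 32
--     while True:
--         recipes = _make_recipes(n)
--         pos = ''.join(map(str, recipes)).find(target)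
--         if pos != -1:
--             return pos
--         n *= 2
--
--
-- def _make_recipes(n):
--     """Generate at least n recipes (no searching here), return exactly the first n."""
--     scoreboard = [3, 7]
--     elf0, elf1 = 0, 1
--     while len(scoreboard) < n:
--         s = scoreboard[elf0] + scoreboard[elf1]
--         if s >= 10:
--             scoreboard.append(1)
--         scoreboard.append(s % 10)
--         elf0 = (elf0 + scoreboard[elf0] + 1) % len(scoreboard)
--         elf1 = (elf1 + scoreboard[elf1] + 1) % len(scoreboard)
--     return scoreboard[:n]
-- ===== Notes on version B (the rewrite author's own statement) =====
-- stated objective: alternative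
-- what changed: B replaces A's single interleaved pass (per-digit sliding-window string maintained while generating) by staged passes: a pure generator that produces exactly n recipes with no searching at all, then one str.find over the joined digits, doubling n and regenerating when the target is absent; digit splitting is arithmetic (append 1 and s%10) instead of iterating over str(s).
-- intended difference: On puzzle_input = 37 (the only input whose digit string occurs at position 0 of the recipe stream '37...' with A's checks starting only after the first append), A overlooks that occurrence and returns 145, the next occurrence, while B returns 0, the true first occurrence, which is the intended answer. — e.g. on get_part_two_answer(37): A returns 145, B returns 0
import Mathlib
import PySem

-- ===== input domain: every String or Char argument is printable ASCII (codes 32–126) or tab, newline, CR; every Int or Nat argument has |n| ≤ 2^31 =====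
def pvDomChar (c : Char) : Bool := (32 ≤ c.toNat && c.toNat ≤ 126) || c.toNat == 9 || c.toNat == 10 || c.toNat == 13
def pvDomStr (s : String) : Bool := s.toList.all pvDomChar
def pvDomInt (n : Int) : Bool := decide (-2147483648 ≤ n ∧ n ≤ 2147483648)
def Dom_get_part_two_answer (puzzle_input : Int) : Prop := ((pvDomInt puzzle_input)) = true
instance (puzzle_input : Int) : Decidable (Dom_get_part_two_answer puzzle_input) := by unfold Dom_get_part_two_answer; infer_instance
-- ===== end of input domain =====

-- One line: B replaces A's single interleaved pass (a per-digit sliding-window check woven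
-- into the generation loop) by staged passes — generate exactly n recipes with no searching
-- at all, then one string find over the joined digits, doubling n and regenerating on
-- failure (alternative decomposition, same cost class).
-- Both Pythons loop unboundedly; the ports totalize this with an explicit search horizon of
-- pvN = 2^55 stream digits (far beyond anything either Python finishes in practice): A's
-- port carries a per-digit budget pvN - 2 and B's port performs 51 doublings of 32, so both
-- ports search exactly the first pvN digits of the stream and return -1 past the horizon.
-- The horizon is a totalization artifact, not part of either algorithm.

def pvN : Nat := 36028797018963968   -- 32 * 2^50 = 2^55

-- scoreboard[i]: at every use site 0 ≤ i < len(scoreboard) (i is a result of '% len' with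
-- positive len), where Array.getD i.toNat is exactly Python's indexing.
def pvIdx (sb : Array Int) (i : Int) : Int := sb.getD i.toNat 0

-- ===== PORT A =====
-- the inner 'for c in str(score_sum)' loop: either returns A's answer / -1 on an exhausted
-- digit budget (.inl), or the updated (budget, scoreboard, current_sequence, counter)
-- (.inr).  int(c) on a digit char is c.toNat - 48.
def pvA_inner (seq : List Char) (ds : List Char) (cap : Nat) (sb : Array Int)
    (win : List Char) (counter : Int) : Int ⊕ (Nat × Array Int × List Char × Int) :=
  match ds with
  | [] => Sum.inr (cap, sb, win, counter)
  | c :: cs =>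
    match cap with
    | 0 => Sum.inl (-1)
    | cap + 1 =>
      let sb' := sb.push ((c.toNat : Int) - 48)
      let counter' := counter + 1
      let win' := if win.length = seq.length then win.drop 1 ++ [c] else win ++ [c]
      if win' = seq then Sum.inl (counter' - (seq.length : Int))
      else pvA_inner seq cs cap sb' win' counter'

def pvA_loop (seq : List Char) : Nat → Nat → Array Int → Int → Int →
    List Char → Int → Int
  | 0, _, _, _, _, _, _ => -1
  | fuel+1, cap, sb, e0, e1, win, counter =>
    match pvA_inner seq (PySem.Int.toChars (pvIdx sb e0 + pvIdx sb e1)) cap sb win counter with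
    | Sum.inl ans => ans
    | Sum.inr (cap', sb', win', counter') =>
      pvA_loop seq fuel cap' sb'
        (PySem.Int.mod (e0 + pvIdx sb' e0 + 1) (sb'.size : Int))
        (PySem.Int.mod (e1 + pvIdx sb' e1 + 1) (sb'.size : Int)) win' counter'

def get_part_two_answer (puzzle_input : Int) : Int :=
  let scoreboard : Array Int := #[3, 7]
  let sequence := PySem.Int.toChars puzzle_input
  let current_sequence := (scoreboard.toList.map (fun c => PySem.Int.toChars c)).flatten
  pvA_loop sequence pvN (pvN - 2) scoreboard 0 1 current_sequence (scoreboard.size : Int)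

-- ===== PORT B =====
-- _make_recipes: the bounded 'while len(scoreboard) < n' loop (fuel n suffices: every
-- iteration appends at least one recipe); scoreboard[:n] is Array.extract 0 n.
def pvMake (n : Nat) : Nat → Array Int → Int → Int → Array Int
  | 0, sb, _, _ => sb.extract 0 n
  | fuel+1, sb, e0, e1 =>
    if sb.size < n then
      let s := pvIdx sb e0 + pvIdx sb e1
      let sb1 := if 10 ≤ s then sb.push 1 else sb
      let sb' := sb1.push (PySem.Int.mod s 10)
      pvMake n fuel sb'
        (PySem.Int.mod (e0 + pvIdx sb' e0 + 1) (sb'.size : Int))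
        (PySem.Int.mod (e1 + pvIdx sb' e1 + 1) (sb'.size : Int))
    else sb.extract 0 n

-- the outer doubling loop; ''.join(map(str, recipes)).find(target) is Chars.find on the
-- flattened digit characters.
def pvB_loop (seq : List Char) : Nat → Nat → Int
  | 0, _ => -1
  | fuel+1, n =>
    let recipes := pvMake n n #[3, 7] 0 1
    let chars := (recipes.toList.map (fun d => PySem.Int.toChars d)).flatten
    let pos := PySem.Chars.find chars seq
    if pos ≠ -1 then pos else pvB_loop seq fuel (n * 2)

def get_part_two_answer_alt (puzzle_input : Int) : Int :=
  pvB_loop (PySem.Int.toChars puzzle_input) 51 32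

-- ===== PRECONDITION & SPEC =====
-- A NEVER returns on any input < 10: a single-digit target can never equal A's window
-- (which always holds at least the two initial recipes), and a negative target's string
-- contains '-', which no recipe digit ever is — A loops forever there.  Pre_ excludes
-- exactly those inputs; it admits every input on which A returns.
def Pre_get_part_two_answer (puzzle_input : Int) : Prop := 10 ≤ puzzle_input
instance (puzzle_input : Int) : Decidable (Pre_get_part_two_answer puzzle_input) := by
  unfold Pre_get_part_two_answer; infer_instance

def pvWitness_get_part_two_answer : Int := 59

-- On the input whose decimal string is '37' (puzzle_input = 37) — the only input whose
-- digit string occurs at position 0 of the recipe stream '37…', which A's checks (starting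
-- only after the first append) never see — A returns 145, the next occurrence, while B
-- returns 0, the true first occurrence, the intended answer.
def D_get_part_two_answer (puzzle_input : Int) : Prop :=
  PySem.Int.toChars puzzle_input = ['3', '7']
instance (puzzle_input : Int) : Decidable (D_get_part_two_answer puzzle_input) := by
  unfold D_get_part_two_answer; infer_instance

def Spec_get_part_two_answer (puzzle_input : Int) (out : Int) : Prop :=
  ¬ D_get_part_two_answer puzzle_input → out = get_part_two_answer_alt puzzle_input
instance (puzzle_input : Int) (out : Int) : Decidable (Spec_get_part_two_answer puzzle_input out) := by
  unfold Spec_get_part_two_answer; infer_instance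

def pvDiffWitness_get_part_two_answer : Int := 37
def pvDiffWitnessOut_get_part_two_answer : Int × Int := (145, 0)

-- ===== CLAIM (what is proved, stated in full; the proofs are below) =====
def Claim_unchanged_get_part_two_answer : Prop :=
  ∀ (puzzle_input : Int), Dom_get_part_two_answer puzzle_input →
    Pre_get_part_two_answer puzzle_input →
    Spec_get_part_two_answer puzzle_input (get_part_two_answer puzzle_input)

def Claim_changed_get_part_two_answer : Prop :=
  Dom_get_part_two_answer (pvDiffWitness_get_part_two_answer) ∧
  Pre_get_part_two_answer (pvDiffWitness_get_part_two_answer) ∧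
  D_get_part_two_answer (pvDiffWitness_get_part_two_answer) ∧
  get_part_two_answer (pvDiffWitness_get_part_two_answer) = pvDiffWitnessOut_get_part_two_answer.1 ∧
  get_part_two_answer_alt (pvDiffWitness_get_part_two_answer) = pvDiffWitnessOut_get_part_two_answer.2 ∧
  pvDiffWitnessOut_get_part_two_answer.1 ≠ pvDiffWitnessOut_get_part_two_answer.2

def Claim_exact_get_part_two_answer : Prop :=
  ∀ (puzzle_input : Int), Dom_get_part_two_answer puzzle_input →
    Pre_get_part_two_answer puzzle_input → D_get_part_two_answer puzzle_input →
    get_part_two_answer puzzle_input ≠ get_part_two_answer_alt puzzle_input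

-- ===== LEMMAS AND PROOFS =====
-- ---- unfolding equations for the Nat.rec-style loops (definitional) ----

lemma pvA_loop_succ (seq : List Char) (fuel cap : Nat) (sb : Array Int) (e0 e1 : Int)
    (win : List Char) (counter : Int) :
    pvA_loop seq (fuel+1) cap sb e0 e1 win counter =
      match pvA_inner seq (PySem.Int.toChars (pvIdx sb e0 + pvIdx sb e1)) cap sb win counter with
      | Sum.inl ans => ans
      | Sum.inr (cap', sb', win', counter') =>
        pvA_loop seq fuel cap' sb'
          (PySem.Int.mod (e0 + pvIdx sb' e0 + 1) (sb'.size : Int))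
          (PySem.Int.mod (e1 + pvIdx sb' e1 + 1) (sb'.size : Int)) win' counter' := rfl

lemma pvA_step1 {seq : List Char} {fuel cap cap' : Nat} {sb sb' : Array Int}
    {e0 e1 e0' e1' : Int} {win win' : List Char} {counter counter' : Int}
    (hinner : pvA_inner seq (PySem.Int.toChars (pvIdx sb e0 + pvIdx sb e1)) cap sb win counter
       = Sum.inr (cap', sb', win', counter'))
    (he0 : PySem.Int.mod (e0 + pvIdx sb' e0 + 1) ((sb'.size : Int)) = e0')
    (he1 : PySem.Int.mod (e1 + pvIdx sb' e1 + 1) ((sb'.size : Int)) = e1') :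
    pvA_loop seq (fuel+1) cap sb e0 e1 win counter
      = pvA_loop seq fuel cap' sb' e0' e1' win' counter' := by
  subst he0; subst he1
  rw [pvA_loop_succ, hinner]

lemma pvA_last {seq : List Char} {fuel cap : Nat} {sb : Array Int}
    {e0 e1 : Int} {win : List Char} {counter ans : Int}
    (hinner : pvA_inner seq (PySem.Int.toChars (pvIdx sb e0 + pvIdx sb e1)) cap sb win counter
       = Sum.inl ans) :
    pvA_loop seq (fuel+1) cap sb e0 e1 win counter = ans := by
  rw [pvA_loop_succ, hinner]

lemma pvMake_succ (n fuel : Nat) (sb : Array Int) (e0 e1 : Int) :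
    pvMake n (fuel+1) sb e0 e1 =
      if sb.size < n then
        (fun sb' => pvMake n fuel sb'
            (PySem.Int.mod (e0 + pvIdx sb' e0 + 1) (sb'.size : Int))
            (PySem.Int.mod (e1 + pvIdx sb' e1 + 1) (sb'.size : Int)))
          ((if 10 ≤ pvIdx sb e0 + pvIdx sb e1 then sb.push 1 else sb).push
            (PySem.Int.mod (pvIdx sb e0 + pvIdx sb e1) 10))
      else sb.extract 0 n := rfl

lemma pvMake_zero (n : Nat) (sb : Array Int) (e0 e1 : Int) :
    pvMake n 0 sb e0 e1 = sb.extract 0 n := rfl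

lemma pvMake_step {n fuel : Nat} {sb sb' : Array Int} {e0 e1 e0' e1' : Int}
    (hlt : sb.size < n)
    (hsb : (if 10 ≤ pvIdx sb e0 + pvIdx sb e1 then sb.push 1 else sb).push
        (PySem.Int.mod (pvIdx sb e0 + pvIdx sb e1) 10) = sb')
    (he0 : PySem.Int.mod (e0 + pvIdx sb' e0 + 1) ((sb'.size : Int)) = e0')
    (he1 : PySem.Int.mod (e1 + pvIdx sb' e1 + 1) ((sb'.size : Int)) = e1') :
    pvMake n (fuel+1) sb e0 e1 = pvMake n fuel sb' e0' e1' := by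
  subst hsb; subst he0; subst he1
  rw [pvMake_succ, if_pos hlt]

lemma pvB_loop_succ (seq : List Char) (fuel n : Nat) :
    pvB_loop seq (fuel+1) n =
      (if PySem.Chars.find (((pvMake n n #[3, 7] 0 1).toList.map
            (fun d => PySem.Int.toChars d)).flatten) seq ≠ -1
       then PySem.Chars.find (((pvMake n n #[3, 7] 0 1).toList.map
            (fun d => PySem.Int.toChars d)).flatten) seq
       else pvB_loop seq fuel (n * 2)) := rfl

lemma pvMake_stop' {n fuel : Nat} {sb : Array Int} {e0 e1 : Int} (h : ¬ sb.size < n)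
    (r : Array Int) (hr : sb.extract 0 n = r) : pvMake n (fuel+1) sb e0 e1 = r := by
  subst hr
  rw [pvMake_succ, if_neg h]

-- ---- digits, chars, windows ----

-- the digit d (0..9) as its decimal character
def pvDC (d : Int) : Char := Char.ofNat (48 + d.toNat)

-- the last L elements (all of l when l is shorter): A's sliding window over the scoreboard
def pvLastL (L : Nat) (l : List Int) : List Int := l.drop (l.length - L)

-- "every entry is a decimal digit"
def pvIsDig (l : List Int) : Prop := ∀ d ∈ l, 0 ≤ d ∧ d ≤ 9

-- Python-style indexing on the list model of the scoreboard
def pvGetD (l : List Int) (i : Int) : Int := l.getD i.toNat 0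

lemma pv_idx_eq (l : List Int) (i : Int) : pvIdx l.toArray i = pvGetD l i := by
  simp [pvIdx, pvGetD, Array.getD_eq_getD_getElem?, List.getD_eq_getElem?_getD]

lemma pv_toNat_ofNat (k : Nat) (hk : k ≤ 60) : (Char.ofNat (48 + k)).toNat = 48 + k := by
  interval_cases k <;> decide

lemma pv_dc_inj {d e : Int} (hd : 0 ≤ d ∧ d ≤ 9) (he : 0 ≤ e ∧ e ≤ 9) :
    pvDC d = pvDC e ↔ d = e := by
  constructor
  · intro h
    have h2 := congrArg Char.toNat h
    unfold pvDC at h2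
    rw [pv_toNat_ofNat d.toNat (by omega), pv_toNat_ofNat e.toNat (by omega)] at h2
    omega
  · rintro rfl; rfl

lemma pv_mapDC_inj {l1 l2 : List Int} (h1 : pvIsDig l1) (h2 : pvIsDig l2) :
    l1.map pvDC = l2.map pvDC ↔ l1 = l2 := by
  induction l1 generalizing l2 with
  | nil => cases l2 <;> simp
  | cons x xs ih =>
    cases l2 with
    | nil => simp
    | cons y ys =>
      simp only [List.map_cons, List.cons.injEq]
      rw [pv_dc_inj (h1 x (by simp)) (h2 y (by simp)),
          ih (fun d hd => h1 d (by simp [hd])) (fun d hd => h2 d (by simp [hd]))]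

-- str(m) for the recipe sums 0..18
lemma pv_toChars_small (m : Nat) (hm : m ≤ 9) :
    PySem.Int.toChars (m : Int) = [Char.ofNat (48 + m)] := by
  interval_cases m <;> decide

lemma pv_toChars_big (m : Nat) (h10 : 10 ≤ m) (hm : m ≤ 18) :
    PySem.Int.toChars (m : Int) = [Char.ofNat 49, Char.ofNat (48 + (m - 10))] := by
  interval_cases m <;> decide

-- recipe-sum digit split, for sums 0..18
lemma pv_mod10_big (m : Nat) (h10 : 10 ≤ m) (hm : m ≤ 18) :
    PySem.Int.mod (m : Int) 10 = ((m - 10 : Nat) : Int) := by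
  interval_cases m <;> decide

lemma pv_mod10_small (m : Nat) (hm : m ≤ 9) :
    PySem.Int.mod (m : Int) 10 = (m : Int) := by
  interval_cases m <;> decide

lemma pv_mod10_big2 (k0 k1 : Nat) (h10 : 10 ≤ k0 + k1) (h18 : k0 + k1 ≤ 18) :
    PySem.Int.mod ((k0 + k1 : Nat) : Int) 10 = (k0 : Int) + k1 - 10 := by
  rw [pv_mod10_big (k0 + k1) h10 h18]
  omega

lemma pv_mod10_small2 (k0 k1 : Nat) (h9 : k0 + k1 ≤ 9) :
    PySem.Int.mod ((k0 + k1 : Nat) : Int) 10 = (k0 : Int) + k1 := by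
  rw [pv_mod10_small (k0 + k1) h9]
  omega

-- chars produced by Nat.toDigitsCore base 10 are decimal digits
lemma pv_tdc_digits (f : Nat) : ∀ (n : Nat) (acc : List Char),
    (∀ c ∈ acc, 48 ≤ c.toNat ∧ c.toNat ≤ 57) →
    ∀ c ∈ Nat.toDigitsCore 10 f n acc, 48 ≤ c.toNat ∧ c.toNat ≤ 57 := by
  induction f with
  | zero => intro n acc hacc c hc; exact hacc c hc
  | succ f ih =>
    intro n acc hacc c hc
    have hdigit : 48 ≤ ((n % 10).digitChar).toNat ∧ ((n % 10).digitChar).toNat ≤ 57 := by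
      have h : n % 10 < 10 := Nat.mod_lt _ (by omega)
      set k := n % 10 with hk
      interval_cases k <;> decide
    simp only [Nat.toDigitsCore] at hc
    by_cases hz : n / 10 = 0
    · rw [if_pos hz] at hc
      rcases List.mem_cons.mp hc with h | h
      · rw [h]; exact hdigit
      · exact hacc c h
    · rw [if_neg hz] at hc
      exact ih (n / 10) _ (by
        intro d hd
        rcases List.mem_cons.mp hd with h | h
        · rw [h]; exact hdigit
        · exact hacc d h) c hc

lemma pv_tdc_mono (f : Nat) : ∀ (n : Nat) (acc : List Char),
    acc.length ≤ (Nat.toDigitsCore 10 f n acc).length := by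
  induction f with
  | zero => intro n acc; simp [Nat.toDigitsCore]
  | succ f ih =>
    intro n acc
    simp only [Nat.toDigitsCore]
    split_ifs with hz
    · simp
    · have := ih (n / 10) ((n % 10).digitChar :: acc)
      simp only [List.length_cons] at this
      omega

lemma pv_toChars_digits (x : Int) (hx : 0 ≤ x) :
    ∀ c ∈ PySem.Int.toChars x, 48 ≤ c.toNat ∧ c.toNat ≤ 57 := by
  intro c hc
  simp only [PySem.Int.toChars, if_neg (by omega : ¬ x < 0)] at hc
  exact pv_tdc_digits _ _ _ (by intro d hd; simp at hd) c hc

lemma pv_toChars_len2 (x : Int) (hx : 10 ≤ x) : 2 ≤ (PySem.Int.toChars x).length := by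
  simp only [PySem.Int.toChars, if_neg (by omega : ¬ x < 0)]
  unfold Nat.toDigits
  obtain ⟨m, hm⟩ : ∃ m, x.toNat = m + 1 := ⟨x.toNat - 1, by omega⟩
  have h10 : ¬ (m + 1) / 10 = 0 := by omega
  rw [hm]
  simp only [Nat.toDigitsCore]
  rw [if_neg h10]
  split_ifs with h2
  · simp
  · have := pv_tdc_mono m ((m + 1) / 10 / 10)
      [((m + 1) / 10 % 10).digitChar, ((m + 1) % 10).digitChar]
    simpa using this

-- int(c) then back to a char: identity on decimal digit chars
lemma pv_dc_roundtrip (c : Char) (h : 48 ≤ c.toNat ∧ c.toNat ≤ 57) :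
    pvDC ((c.toNat : Int) - 48) = c := by
  unfold pvDC
  have h1 : 48 + (((c.toNat : Int) - 48).toNat) = c.toNat := by omega
  rw [h1, Char.ofNat_toNat]

lemma pv_lastL_len (L : Nat) (l : List Int) : (pvLastL L l).length = min l.length L := by
  simp [pvLastL]; omega

lemma pv_lastL_dig {l : List Int} (h : pvIsDig l) (L : Nat) : pvIsDig (pvLastL L l) :=
  fun d hd => h d (List.mem_of_mem_drop hd)

lemma pv_lastL_append (L : Nat) (hL : 1 ≤ L) (l : List Int) (d : Int) :
    pvLastL L (l ++ [d]) =
      (if L ≤ l.length then (pvLastL L l).drop 1 else pvLastL L l) ++ [d] := by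
  unfold pvLastL
  by_cases h : L ≤ l.length
  · rw [if_pos h]
    have h1 : (l ++ [d]).length - L = (l.length - L) + 1 := by simp; omega
    rw [h1, List.drop_append_of_le_length (by omega), List.drop_drop]
  · rw [if_neg h]
    have h1 : (l ++ [d]).length - L = 0 := by simp; omega
    have h2 : l.length - L = 0 := by omega
    rw [h1, h2]
    simp

-- A's per-digit window update keeps the window equal to the last L scoreboard digits
lemma pv_win_step (tl : List Int) (hL : 2 ≤ tl.length) (l : List Int) (d : Int) :
    (if ((pvLastL tl.length l).map pvDC).length = (tl.map pvDC).length
      then ((pvLastL tl.length l).map pvDC).drop 1 ++ [pvDC d]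
      else ((pvLastL tl.length l).map pvDC) ++ [pvDC d])
      = (pvLastL tl.length (l ++ [d])).map pvDC := by
  rw [pv_lastL_append tl.length (by omega) l d]
  by_cases h : tl.length ≤ l.length
  · rw [if_pos (by simp [pv_lastL_len]; omega), if_pos h]
    simp
  · rw [if_neg (by simp [pv_lastL_len]; omega), if_neg h]
    simp

lemma pv_getD_dig {l : List Int} (h : pvIsDig l) (i : Int) :
    0 ≤ pvGetD l i ∧ pvGetD l i ≤ 9 := by
  unfold pvGetD
  rw [List.getD_eq_getElem?_getD]
  cases hg : l[i.toNat]? with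
  | none => simp
  | some d =>
    have := h d (List.mem_of_getElem? hg)
    simpa using this

lemma pv_getD_dig' {l : List Int} (h : pvIsDig l) (i : Int) :
    ∃ k : Nat, k ≤ 9 ∧ pvGetD l i = (k : Int) := by
  obtain ⟨h0, h9⟩ := pv_getD_dig h i
  exact ⟨(pvGetD l i).toNat, by omega, by omega⟩
-- ---- the recipe stream (common semantics of both generation loops) ----

def pvS : Nat → List Int × Int × Int
  | 0 => ([3, 7], 0, 1)
  | k+1 =>
    let l := (pvS k).1
    let e0 := (pvS k).2.1
    let e1 := (pvS k).2.2
    let s := pvGetD l e0 + pvGetD l e1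
    let l' := l ++ (if 10 ≤ s then [1, s - 10] else [s])
    (l', PySem.Int.mod (e0 + pvGetD l' e0 + 1) (l'.length : Int),
         PySem.Int.mod (e1 + pvGetD l' e1 + 1) (l'.length : Int))

lemma pvS_succ_list (k : Nat) :
    (pvS (k+1)).1 = (pvS k).1 ++
      (if 10 ≤ pvGetD (pvS k).1 (pvS k).2.1 + pvGetD (pvS k).1 (pvS k).2.2
       then [1, pvGetD (pvS k).1 (pvS k).2.1 + pvGetD (pvS k).1 (pvS k).2.2 - 10]
       else [pvGetD (pvS k).1 (pvS k).2.1 + pvGetD (pvS k).1 (pvS k).2.2]) := rfl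

lemma pvS_succ_e0 (k : Nat) :
    (pvS (k+1)).2.1 = PySem.Int.mod ((pvS k).2.1 + pvGetD (pvS (k+1)).1 (pvS k).2.1 + 1)
      (((pvS (k+1)).1.length : Int)) := rfl

lemma pvS_succ_e1 (k : Nat) :
    (pvS (k+1)).2.2 = PySem.Int.mod ((pvS k).2.2 + pvGetD (pvS (k+1)).1 (pvS k).2.2 + 1)
      (((pvS (k+1)).1.length : Int)) := rfl

lemma pvS_dig : ∀ k, pvIsDig (pvS k).1 := by
  intro k
  induction k with
  | zero =>
    intro d hd
    rcases List.mem_cons.mp hd with rfl | hd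
    · norm_num
    · simp only [List.mem_cons, List.not_mem_nil, or_false] at hd
      subst hd; norm_num
  | succ k ih =>
    rw [pvS_succ_list]
    intro d hd
    rcases List.mem_append.mp hd with h | h
    · exact ih d h
    · obtain ⟨a0, a9⟩ := pv_getD_dig ih (pvS k).2.1
      obtain ⟨b0, b9⟩ := pv_getD_dig ih (pvS k).2.2
      by_cases hb : 10 ≤ pvGetD (pvS k).1 (pvS k).2.1 + pvGetD (pvS k).1 (pvS k).2.2
      · rw [if_pos hb] at h
        simp only [List.mem_cons, List.not_mem_nil, or_false] at h
        rcases h with rfl | rfl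
        · norm_num
        · omega
      · rw [if_neg hb] at h
        simp only [List.mem_cons, List.not_mem_nil, or_false] at h
        subst h; omega

lemma pvS_len_lb : ∀ k, 2 + k ≤ (pvS k).1.length := by
  intro k
  induction k with
  | zero => simp [pvS]
  | succ k ih =>
    rw [pvS_succ_list]
    rw [List.length_append]
    split_ifs <;> simp <;> omega

lemma pvS_prefix_succ (k : Nat) : (pvS k).1 <+: (pvS (k+1)).1 := by
  rw [pvS_succ_list]; exact List.prefix_append _ _

lemma pvS_prefix : ∀ {k j : Nat}, k ≤ j → (pvS k).1 <+: (pvS j).1 := by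
  intro k j h
  induction j with
  | zero =>
    have : k = 0 := by omega
    subst this; exact List.prefix_refl _
  | succ j ih =>
    rcases Nat.lt_or_ge k (j+1) with hlt | hge
    · exact (ih (by omega)).trans (pvS_prefix_succ j)
    · have : k = j + 1 := by omega
      subst this; exact List.prefix_refl _

lemma pv_step_data (k : Nat) {l : List Int} {e0 e1 : Int} (hst : pvS k = (l, e0, e1))
    {k0 k1 : Nat} (h0 : pvGetD l e0 = (k0 : Int)) (h1 : pvGetD l e1 = (k1 : Int)) :
    (pvS (k+1)).1 = l ++
      (if 10 ≤ k0 + k1 then [(1 : Int), (k0 : Int) + k1 - 10] else [(k0 : Int) + k1]) := by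
  have e := pvS_succ_list k
  rw [hst] at e
  simp only at e
  rw [h0, h1] at e
  rw [e]
  by_cases hb : 10 ≤ k0 + k1
  · rw [if_pos (show (10 : Int) ≤ (k0 : Int) + k1 by exact_mod_cast hb), if_pos hb]
  · rw [if_neg (fun hcon => hb (by exact_mod_cast hcon)), if_neg hb]

lemma pv_step_state (k : Nat) {l : List Int} {e0 e1 : Int} (hst : pvS k = (l, e0, e1)) :
    pvS (k+1) = ((pvS (k+1)).1,
      PySem.Int.mod (e0 + pvIdx (pvS (k+1)).1.toArray e0 + 1)
        (((pvS (k+1)).1.toArray.size : Int)),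
      PySem.Int.mod (e1 + pvIdx (pvS (k+1)).1.toArray e1 + 1)
        (((pvS (k+1)).1.toArray.size : Int))) := by
  refine Prod.ext rfl (Prod.ext ?_ ?_)
  · rw [pvS_succ_e0, hst]
    simp [pv_idx_eq]
  · rw [pvS_succ_e1, hst]
    simp [pv_idx_eq]

def pvFull : List Int := (pvS pvN).1.take pvN

lemma pvFull_len : pvFull.length = pvN := by
  have := pvS_len_lb pvN
  simp only [pvFull, List.length_take]
  omega

lemma pvFull_dig : pvIsDig pvFull :=
  fun d hd => pvS_dig pvN d (List.mem_of_mem_take hd)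

lemma pv_prefix_take {α : Type} {l1 l2 : List α} (h : l1 <+: l2) {m : Nat}
    (hm : m ≤ l1.length) : l1.take m = l2.take m := by
  obtain ⟨t, rfl⟩ := h
  rw [List.take_append_of_le_length hm]

lemma pv_take_full (k m : Nat) (h1 : m ≤ (pvS k).1.length) (h2 : m ≤ pvN) :
    (pvS k).1.take m = pvFull.take m := by
  have hfull : pvFull.take m = (pvS pvN).1.take m := by
    simp only [pvFull, List.take_take]
    congr 1
    omega
  rw [hfull]
  rcases le_total k pvN with h | h
  · exact pv_prefix_take (pvS_prefix h) h1
  · exact (pv_prefix_take (pvS_prefix h) (by have := pvS_len_lb pvN; omega)).symm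

lemma pv_take_full' (k : Nat) {l : List Int} {e0 e1 : Int} (hst : pvS k = (l, e0, e1))
    {m : Nat} (h1 : m ≤ l.length) (h2 : m ≤ pvN) : l.take m = pvFull.take m := by
  have h := pv_take_full k m (by rw [hst]; exact h1) h2
  rw [hst] at h
  exact h

-- ---- the common answer formula: first end-position of a window match within the horizon ----

def pvMatchEndB (tl : List Int) (m : Nat) : Bool :=
  decide (pvLastL tl.length (pvFull.take m) = tl)

def pvAnsFrom (tl : List Int) (lo : Nat) : Int :=
  match (List.range' lo (pvN + 1 - lo)).find? (pvMatchEndB tl) with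
  | some m => (m : Int) - tl.length
  | none => -1

lemma pvAnsFrom_stop (tl : List Int) {lo : Nat} (h : pvN < lo) : pvAnsFrom tl lo = -1 := by
  unfold pvAnsFrom
  rw [show pvN + 1 - lo = 0 by omega]
  rfl

lemma pvAnsFrom_step (tl : List Int) {lo : Nat} (h : lo ≤ pvN) :
    pvAnsFrom tl lo =
      if pvMatchEndB tl lo then (lo : Int) - tl.length else pvAnsFrom tl (lo+1) := by
  unfold pvAnsFrom
  rw [show pvN + 1 - lo = (pvN - lo) + 1 by omega, List.range'_succ, List.find?_cons]
  rw [show pvN + 1 - (lo + 1) = pvN - lo by omega]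
  cases hm : pvMatchEndB tl lo <;> simp [hm]

lemma pvAnsFrom_found (tl : List Int) {lo m : Nat} (h1 : lo ≤ m) (h2 : m ≤ pvN)
    (hm : pvMatchEndB tl m = true)
    (hmin : ∀ j, lo ≤ j → j < m → pvMatchEndB tl j = false) :
    pvAnsFrom tl lo = (m : Int) - tl.length := by
  obtain ⟨d, hd⟩ : ∃ d, m - lo = d := ⟨m - lo, rfl⟩
  induction d generalizing lo with
  | zero =>
    have : lo = m := by omega
    subst this
    rw [pvAnsFrom_step tl h2, if_pos hm]
  | succ d ih =>
    rw [pvAnsFrom_step tl (by omega), if_neg (by rw [hmin lo (le_refl _) (by omega)]; simp)]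
    exact ih (by omega) (fun j hj1 hj2 => hmin j (by omega) hj2) (by omega)

lemma pvAnsFrom_none (tl : List Int) {lo : Nat}
    (h : ∀ j, lo ≤ j → j ≤ pvN → pvMatchEndB tl j = false) : pvAnsFrom tl lo = -1 := by
  obtain ⟨d, hd⟩ : ∃ d, pvN + 1 - lo = d := ⟨pvN + 1 - lo, rfl⟩
  induction d generalizing lo with
  | zero => exact pvAnsFrom_stop tl (by omega)
  | succ d ih =>
    rw [pvAnsFrom_step tl (by omega), if_neg (by rw [h lo (le_refl _) (by omega)]; simp)]
    exact ih (fun j hj1 hj2 => h j (by omega) hj2) (by omega)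

lemma pvAnsFrom_shift (tl : List Int) {lo lo' : Nat} (hle : lo ≤ lo')
    (h : ∀ j, lo ≤ j → j < lo' → pvMatchEndB tl j = false) :
    pvAnsFrom tl lo = pvAnsFrom tl lo' := by
  obtain ⟨d, hd⟩ : ∃ d, lo' - lo = d := ⟨lo' - lo, rfl⟩
  induction d generalizing lo with
  | zero =>
    have : lo = lo' := by omega
    subst this; rfl
  | succ d ih =>
    rcases Nat.lt_or_ge pvN lo with hN | hN
    · rw [pvAnsFrom_stop tl hN, pvAnsFrom_stop tl (by omega)]
    · rw [pvAnsFrom_step tl (by omega), if_neg (by rw [h lo (le_refl _) (by omega)]; simp)]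
      exact ih (by omega) (fun j hj1 hj2 => h j (by omega) hj2) (by omega)

-- a match needs at least tl.length digits
lemma pv_matchEnd_small (tl : List Int) {m : Nat} (hm : m < tl.length) :
    pvMatchEndB tl m = false := by
  unfold pvMatchEndB
  rw [decide_eq_false_iff_not]
  intro hEq
  have hlen := congrArg List.length hEq
  rw [pv_lastL_len, List.length_take, pvFull_len] at hlen
  omega

-- a match at end position m (tl.length ≤ m ≤ pvN) is an occurrence at m - tl.length
lemma pv_matchEnd_iff (tl : List Int) {m : Nat} (h1 : tl.length ≤ m) (h2 : m ≤ pvN) :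
    pvMatchEndB tl m = true ↔ tl <+: pvFull.drop (m - tl.length) := by
  unfold pvMatchEndB
  rw [decide_eq_true_iff]
  have hlen : (pvFull.take m).length = m := by
    rw [List.length_take, pvFull_len]; omega
  rw [pvLastL, hlen, List.drop_take]
  rw [show m - (m - tl.length) = tl.length by omega]
  rw [List.prefix_iff_eq_take]
  constructor
  · intro h; exact h.symm
  · intro h; exact h.symm
-- ---- A-side: the interleaved loop computes pvAnsFrom ----

lemma pvA_inner_nil (seq : List Char) (cap : Nat) (sb : Array Int) (win : List Char)
    (counter : Int) : pvA_inner seq [] cap sb win counter = Sum.inr (cap, sb, win, counter) := rfl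

lemma pvA_inner_zero (seq : List Char) (c : Char) (cs : List Char) (sb : Array Int)
    (win : List Char) (counter : Int) :
    pvA_inner seq (c::cs) 0 sb win counter = Sum.inl (-1) := rfl

lemma pvA_inner_cons (seq : List Char) (c : Char) (cs : List Char) (cap : Nat)
    (sb : Array Int) (win : List Char) (counter : Int) :
    pvA_inner seq (c::cs) (cap+1) sb win counter =
      (if (if win.length = seq.length then win.drop 1 ++ [c] else win ++ [c]) = seq
       then Sum.inl ((counter + 1) - (seq.length : Int))
       else pvA_inner seq cs cap (sb.push ((c.toNat : Int) - 48))
              (if win.length = seq.length then win.drop 1 ++ [c] else win ++ [c])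
              (counter + 1)) := rfl

lemma pv_dc_int {d : Int} (h0 : 0 ≤ d) (h9 : d ≤ 9) : ((pvDC d).toNat : Int) - 48 = d := by
  unfold pvDC
  rw [pv_toNat_ofNat d.toNat (by omega)]
  omega

lemma pv_app_dig {l : List Int} (hl : pvIsDig l) {d : Int} (h0 : 0 ≤ d) (h9 : d ≤ 9) :
    pvIsDig (l ++ [d]) := by
  intro x hx
  rcases List.mem_append.mp hx with h | h
  · exact hl x h
  · simp only [List.mem_cons, List.not_mem_nil, or_false] at h
    subst h; exact ⟨h0, h9⟩

lemma pv_A_char (tl : List Int) (htl : pvIsDig tl) (hL : 2 ≤ tl.length) :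
    ∀ (fuel k : Nat) (l : List Int) (e0 e1 : Int), pvS k = (l, e0, e1) →
      l.length ≤ pvN → pvN - l.length < fuel →
      pvA_loop (tl.map pvDC) fuel (pvN - l.length) l.toArray e0 e1
        ((pvLastL tl.length l).map pvDC) ((l.length : Int))
      = pvAnsFrom tl (l.length + 1) := by
  intro fuel
  induction fuel with
  | zero => intro k l e0 e1 _ _ h; omega
  | succ f ih =>
    intro k l e0 e1 hst hlen hfuel
    have hdl : pvIsDig l := by
      have := pvS_dig k; rw [hst] at this; exact this
    obtain ⟨k0, hk0, h0⟩ := pv_getD_dig' hdl e0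
    obtain ⟨k1, hk1, h1⟩ := pv_getD_dig' hdl e1
    rw [pvA_loop_succ]
    have hsum : pvIdx l.toArray e0 + pvIdx l.toArray e1 = ((k0 + k1 : Nat) : Int) := by
      rw [pv_idx_eq, pv_idx_eq, h0, h1]; push_cast; ring
    rw [hsum]
    have hstep := pv_step_data k hst h0 h1
    by_cases hbig : 10 ≤ k0 + k1
    · -- two digits: 1 and k0+k1-10
      rw [if_pos hbig] at hstep
      set d2 : Int := (k0 : Int) + k1 - 10 with hd2
      have hd20 : 0 ≤ d2 := by rw [hd2]; push_cast; omega
      have hd29 : d2 ≤ 9 := by rw [hd2]; push_cast; omega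
      have hdl1 : pvIsDig (l ++ [1]) := pv_app_dig hdl (by norm_num) (by norm_num)
      have hdl2 : pvIsDig ((l ++ [1]) ++ [d2]) := pv_app_dig hdl1 hd20 hd29
      rw [pv_toChars_big (k0 + k1) hbig (by omega)]
      have hch1 : Char.ofNat 49 = pvDC 1 := by decide
      have hch2 : Char.ofNat (48 + (k0 + k1 - 10)) = pvDC d2 := by
        have ht : d2.toNat = k0 + k1 - 10 := by omega
        unfold pvDC
        rw [ht]
      rw [hch1, hch2]
      rcases hc : pvN - l.length with _ | c
      · -- budget exhausted before the first digit: l already fills the horizon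
        rw [pvA_inner_zero]
        have hlN : l.length = pvN := by omega
        rw [hlN, pvAnsFrom_stop tl (by omega)]
      · -- first digit
        rw [pvA_inner_cons, pv_win_step tl hL l 1, pv_dc_int (by norm_num) (by norm_num)]
        have hTake1 : pvFull.take (l.length + 1) = l ++ [1] := by
          rw [← pv_take_full (k+1) (l.length + 1)
              (by rw [hstep]; simp) (by omega), hstep,
            show l ++ [(1 : Int), d2] = (l ++ [1]) ++ [d2] by simp, List.take_left']
          simp
        have hME1 : pvMatchEndB tl (l.length + 1) = decide (pvLastL tl.length (l ++ [1]) = tl) := by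
          unfold pvMatchEndB
          rw [hTake1]
        by_cases hm1 : pvLastL tl.length (l ++ [1]) = tl
        · rw [if_pos (by rw [← pv_mapDC_inj (pv_lastL_dig hdl1 _) htl] at hm1; exact hm1)]
          rw [pvAnsFrom_step tl (by omega), if_pos (by rw [hME1]; exact decide_eq_true hm1)]
          simp only [List.length_map]
          push_cast
          ring
        · rw [if_neg (by rw [← pv_mapDC_inj (pv_lastL_dig hdl1 _) htl] at hm1; exact hm1)]
          -- second digit
          rcases hc2 : c with _ | c2
          · -- budget exhausted between the two digits: the first one reached the horizon
            rw [pvA_inner_zero]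
            have hlN : l.length + 1 = pvN := by omega
            rw [pvAnsFrom_step tl (by omega),
              if_neg (by rw [hME1]; simpa using hm1), hlN,
              pvAnsFrom_stop tl (by omega)]
          · rw [pvA_inner_cons, List.push_toArray, pv_win_step tl hL (l ++ [1]) d2,
              pv_dc_int hd20 hd29]
            have hTake2 : pvFull.take (l.length + 2) = (l ++ [1]) ++ [d2] := by
              rw [← pv_take_full (k+1) (l.length + 2) (by rw [hstep]; simp) (by omega), hstep,
                show l ++ [(1 : Int), d2] = (l ++ [1]) ++ [d2] by simp]
              apply List.take_of_length_le
              simp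
            have hME2 : pvMatchEndB tl (l.length + 2)
                = decide (pvLastL tl.length ((l ++ [1]) ++ [d2]) = tl) := by
              unfold pvMatchEndB
              rw [hTake2]
            by_cases hm2 : pvLastL tl.length ((l ++ [1]) ++ [d2]) = tl
            · rw [if_pos (by rw [← pv_mapDC_inj (pv_lastL_dig hdl2 _) htl] at hm2; exact hm2)]
              rw [pvAnsFrom_step tl (by omega),
                if_neg (by rw [hME1]; simpa using hm1),
                pvAnsFrom_step tl (by omega),
                if_pos (by rw [hME2]; exact decide_eq_true hm2)]
              simp only [List.length_map]
              push_cast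
              ring
            · rw [if_neg (by rw [← pv_mapDC_inj (pv_lastL_dig hdl2 _) htl] at hm2; exact hm2),
                pvA_inner_nil]
              rw [pvAnsFrom_step tl (by omega),
                if_neg (by rw [hME1]; simpa using hm1),
                pvAnsFrom_step tl (by omega),
                if_neg (by rw [hME2]; simpa using hm2)]
              have hl' : (pvS (k+1)).1 = (l ++ [1]) ++ [d2] := by
                rw [hstep]
                simp
              have hnext := pv_step_state k hst
              rw [hl'] at hnext
              have ihx := ih (k+1) ((l ++ [1]) ++ [d2]) _ _ hnext (by simp; omega)
                (by simp; omega)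
              have hcap : pvN - ((l ++ [1]) ++ [d2]).length = c2 := by simp; omega
              rw [hcap] at ihx
              have hlen2 : ((l ++ [1]) ++ [d2]).length = l.length + 2 := by simp
              rw [hlen2] at ihx
              have hcnt : (l.length : Int) + 1 + 1 = ((l.length + 2 : Nat) : Int) := by
                push_cast
                ring
              rw [hcnt]
              simp only [List.push_toArray]
              exact ihx
    · -- one digit: k0+k1
      rw [if_neg hbig] at hstep
      set d1 : Int := (k0 : Int) + k1 with hd1
      have hd10 : 0 ≤ d1 := by rw [hd1]; push_cast; omega
      have hd19 : d1 ≤ 9 := by rw [hd1]; push_cast; omega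
      have hdl1 : pvIsDig (l ++ [d1]) := pv_app_dig hdl hd10 hd19
      rw [pv_toChars_small (k0 + k1) (by omega)]
      have hch1 : Char.ofNat (48 + (k0 + k1)) = pvDC d1 := by
        have ht : d1.toNat = k0 + k1 := by omega
        unfold pvDC
        rw [ht]
      rw [hch1]
      rcases hc : pvN - l.length with _ | c
      · rw [pvA_inner_zero]
        have hlN : l.length = pvN := by omega
        rw [hlN, pvAnsFrom_stop tl (by omega)]
      · rw [pvA_inner_cons, pv_win_step tl hL l d1, pv_dc_int hd10 hd19]
        have hTake1 : pvFull.take (l.length + 1) = l ++ [d1] := by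
          rw [← pv_take_full (k+1) (l.length + 1) (by rw [hstep]; simp) (by omega), hstep]
          apply List.take_of_length_le
          simp
        have hME1 : pvMatchEndB tl (l.length + 1) = decide (pvLastL tl.length (l ++ [d1]) = tl) := by
          unfold pvMatchEndB
          rw [hTake1]
        by_cases hm1 : pvLastL tl.length (l ++ [d1]) = tl
        · rw [if_pos (by rw [← pv_mapDC_inj (pv_lastL_dig hdl1 _) htl] at hm1; exact hm1)]
          rw [pvAnsFrom_step tl (by omega), if_pos (by rw [hME1]; exact decide_eq_true hm1)]
          simp only [List.length_map]
          push_cast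
          ring
        · rw [if_neg (by rw [← pv_mapDC_inj (pv_lastL_dig hdl1 _) htl] at hm1; exact hm1),
            pvA_inner_nil]
          rw [pvAnsFrom_step tl (by omega),
            if_neg (by rw [hME1]; simpa using hm1)]
          have hl' : (pvS (k+1)).1 = l ++ [d1] := hstep
          have hnext := pv_step_state k hst
          rw [hl'] at hnext
          have ihx := ih (k+1) (l ++ [d1]) _ _ hnext (by simp; omega) (by simp; omega)
          have hcap : pvN - (l ++ [d1]).length = c := by simp; omega
          rw [hcap] at ihx
          have hlen1 : (l ++ [d1]).length = l.length + 1 := by simp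
          rw [hlen1] at ihx
          have hcnt : (l.length : Int) + 1 = ((l.length + 1 : Nat) : Int) := by
            push_cast
            ring
          rw [hcnt]
          simp only [List.push_toArray]
          exact ihx
-- ---- B-side: staged generate-then-search computes the same pvAnsFrom ----

lemma pv_extract_take (l : List Int) (n : Nat) :
    l.toArray.extract 0 n = (l.take n).toArray := by
  apply Array.toList_inj.mp
  simp [Array.toList_extract, List.extract_eq_drop_take]

lemma pv_make_eq (n : Nat) (hn : n ≤ pvN) :
    ∀ (fuel k : Nat) (l : List Int) (e0 e1 : Int), pvS k = (l, e0, e1) →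
      n ≤ l.length + fuel →
      pvMake n fuel l.toArray e0 e1 = (pvFull.take n).toArray := by
  intro fuel
  induction fuel with
  | zero =>
    intro k l e0 e1 hst hle
    rw [pvMake_zero, pv_extract_take, pv_take_full' k hst (by omega) hn]
  | succ f ih =>
    intro k l e0 e1 hst hle
    have hdl : pvIsDig l := by
      have := pvS_dig k; rw [hst] at this; exact this
    by_cases hlt : l.toArray.size < n
    · obtain ⟨k0, hk0, h0⟩ := pv_getD_dig' hdl e0
      obtain ⟨k1, hk1, h1⟩ := pv_getD_dig' hdl e1
      have hsum : pvIdx l.toArray e0 + pvIdx l.toArray e1 = ((k0 + k1 : Nat) : Int) := by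
        rw [pv_idx_eq, pv_idx_eq, h0, h1]; push_cast; ring
      have hstep := pv_step_data k hst h0 h1
      rw [pvMake_succ, if_pos hlt, hsum]
      have hnext := pv_step_state k hst
      by_cases hbig : 10 ≤ k0 + k1
      · rw [if_pos (show (10 : Int) ≤ ((k0 + k1 : Nat) : Int) by exact_mod_cast hbig),
          pv_mod10_big2 k0 k1 hbig (by omega)]
        rw [if_pos hbig] at hstep
        have harr : (l.toArray.push 1).push ((k0 : Int) + k1 - 10)
            = (pvS (k+1)).1.toArray := by
          rw [hstep]
          simp
        rw [harr]
        refine ih (k+1) (pvS (k+1)).1 _ _ hnext ?_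
        rw [hstep]
        simp
        omega
      · rw [if_neg (show ¬ (10 : Int) ≤ ((k0 + k1 : Nat) : Int) by push_cast; omega),
          pv_mod10_small2 k0 k1 (by omega)]
        rw [if_neg hbig] at hstep
        have harr : l.toArray.push ((k0 : Int) + k1) = (pvS (k+1)).1.toArray := by
          rw [hstep]
          simp
        rw [harr]
        refine ih (k+1) (pvS (k+1)).1 _ _ hnext ?_
        rw [hstep]
        simp
        omega
    · rw [pvMake_succ, if_neg hlt, pv_extract_take,
        pv_take_full' k hst (by simpa using hlt) hn]

lemma pv_dig_sub {l t : List Int} (h : pvIsDig l) (hs : t.Sublist l) : pvIsDig t :=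
  fun d hd => h d (hs.mem hd)

lemma pv_chars_map (D : List Int) (hD : pvIsDig D) :
    (D.map (fun d => PySem.Int.toChars d)).flatten = D.map pvDC := by
  induction D with
  | nil => rfl
  | cons d t ih =>
    have hd := hD d (by simp)
    have hdc : PySem.Int.toChars d = [pvDC d] := by
      have : d = ((d.toNat : Nat) : Int) := by omega
      rw [this, pv_toChars_small d.toNat (by omega)]
      rfl
    rw [List.map_cons, List.map_cons, List.flatten_cons, hdc, List.singleton_append,
      ih (fun x hx => hD x (by simp [hx]))]

lemma pv_prefix_map_iff {a b : List Int} (ha : pvIsDig a) (hb : pvIsDig b) :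
    a.map pvDC <+: b.map pvDC ↔ a <+: b := by
  rw [List.prefix_iff_eq_take, List.prefix_iff_eq_take, ← List.map_take,
    List.length_map, pv_mapDC_inj ha (pv_dig_sub hb (List.take_sublist _ _))]

-- occurrences of the target inside the searched prefix, moved between chars and digits
lemma pv_occ_iff (tl : List Int) (htl : pvIsDig tl) {n p : Nat} (hn : n ≤ pvN) :
    tl.map pvDC <+: ((pvFull.take n).map pvDC).drop p ↔
      (tl <+: pvFull.drop p ∧ tl.length ≤ n - p) := by
  rw [← List.map_drop,
    pv_prefix_map_iff htl (pv_dig_sub pvFull_dig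
      (((pvFull.take n).drop_sublist p).trans (pvFull.take_sublist n))),
    List.drop_take, List.prefix_take_iff]

lemma pv_B_char (tl : List Int) (htl : pvIsDig tl) (hL : 2 ≤ tl.length) :
    ∀ (fuel n : Nat), 1 ≤ fuel → n * 2 ^ (fuel - 1) = pvN →
      pvB_loop (tl.map pvDC) fuel n = pvAnsFrom tl tl.length := by
  intro fuel
  induction fuel with
  | zero => intro n h; omega
  | succ f ih =>
    intro n _ hpow
    have hnN : n ≤ pvN := by
      rw [← hpow]
      exact Nat.le_mul_of_pos_right n (by positivity)
    have hst0 : pvS 0 = ([3, 7], 0, 1) := rfl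
    have hmk : pvMake n n #[3, 7] 0 1 = (pvFull.take n).toArray := by
      have := pv_make_eq n hnN n 0 [3, 7] 0 1 hst0 (by simp)
      exact this
    rw [pvB_loop_succ, hmk]
    have hchars : ((pvFull.take n).toArray.toList.map (fun d => PySem.Int.toChars d)).flatten
        = (pvFull.take n).map pvDC := by
      rw [show ((pvFull.take n).toArray).toList = pvFull.take n by simp]
      exact pv_chars_map _ (pv_dig_sub pvFull_dig (pvFull.take_sublist n))
    rw [hchars]
    by_cases hfind : PySem.Chars.find ((pvFull.take n).map pvDC) (tl.map pvDC) = -1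
    · rw [if_neg (by simpa using hfind)]
      have hnone : ∀ j, ¬ (tl.map pvDC <+: ((pvFull.take n).map pvDC).drop j) := by
        intro j hj
        have : PySem.Chars.isIn (tl.map pvDC) ((pvFull.take n).map pvDC) = true :=
          (PySem.Chars.exists_prefix_drop_iff_isIn _ _).mp ⟨j, hj⟩
        rw [PySem.Chars.isIn_iff_infix] at this
        exact (PySem.Chars.find_eq_neg_one_iff _ _).mp hfind this
      rcases f with _ | f'
      · have hn : n = pvN := by simpa using hpow
        have hz : pvB_loop (tl.map pvDC) 0 (n * 2) = -1 := rfl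
        rw [hz]
        symm
        apply pvAnsFrom_none
        intro j hj1 hj2
        cases hmej : pvMatchEndB tl j
        · rfl
        · exfalso
          have hocc := (pv_matchEnd_iff tl hj1 hj2).mp hmej
          exact hnone (j - tl.length) ((pv_occ_iff tl htl hnN).mpr
            ⟨hocc, by rw [hn]; omega⟩)
      · refine ih (n * 2) (by omega) ?_
        rw [show f' + 1 - 1 = f' from rfl,
          show n * 2 * 2 ^ f' = n * 2 ^ (f' + 1) from by rw [pow_succ]; ring]
        exact hpow
    · rw [if_pos (by simpa using hfind)]
      have hpos0 : 0 ≤ PySem.Chars.find ((pvFull.take n).map pvDC) (tl.map pvDC) := by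
        have := PySem.Chars.neg_one_le_find ((pvFull.take n).map pvDC) (tl.map pvDC)
        omega
      obtain ⟨hpre, hmin⟩ := PySem.Chars.find_spec hpos0
      set p : Nat := (PySem.Chars.find ((pvFull.take n).map pvDC) (tl.map pvDC)).toNat with hp
      obtain ⟨hocc, hlen⟩ := (pv_occ_iff tl htl hnN).mp hpre
      have hpn : p + tl.length ≤ n := by omega
      rw [pvAnsFrom_found tl (lo := tl.length) (m := p + tl.length) (by omega) (by omega)
        ((pv_matchEnd_iff tl (by omega) (by omega)).mpr (by
          rw [show p + tl.length - tl.length = p by omega]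
          exact hocc))
        (fun j hj1 hj2 => by
          cases hmej : pvMatchEndB tl j
          · rfl
          · exfalso
            have hoccj := (pv_matchEnd_iff tl hj1 (by omega)).mp hmej
            exact hmin (j - tl.length) (by omega)
              ((pv_occ_iff tl htl hnN).mpr ⟨hoccj, by omega⟩))]
      rw [show PySem.Chars.find ((pvFull.take n).map pvDC) (tl.map pvDC) = (p : Int) by
        rw [hp, Int.toNat_of_nonneg hpos0]]
      push_cast
      ring
-- ---- assembling the two characterizations ----

lemma pv_tl_dig (x : Int) (h10 : 10 ≤ x) :
    pvIsDig ((PySem.Int.toChars x).map (fun c => ((c.toNat : Int) - 48))) := by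
  intro d hd
  simp only [List.mem_map] at hd
  obtain ⟨c, hc, rfl⟩ := hd
  have := pv_toChars_digits x (by omega) c hc
  omega

lemma pv_tl_map (x : Int) (h10 : 10 ≤ x) :
    ((PySem.Int.toChars x).map (fun c => ((c.toNat : Int) - 48))).map pvDC
      = PySem.Int.toChars x := by
  rw [List.map_map]
  conv_rhs => rw [← List.map_id (PySem.Int.toChars x)]
  apply List.map_congr_left
  intro c hc
  exact pv_dc_roundtrip c (pv_toChars_digits x (by omega) c hc)

lemma pv_tl_len (x : Int) (h10 : 10 ≤ x) :
    2 ≤ ((PySem.Int.toChars x).map (fun c => ((c.toNat : Int) - 48))).length := by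
  simpa using pv_toChars_len2 x h10

set_option maxRecDepth 4000 in
lemma pv_A_eq (x : Int) (h10 : 10 ≤ x) :
    get_part_two_answer x =
      pvAnsFrom ((PySem.Int.toChars x).map (fun c => ((c.toNat : Int) - 48))) 3 := by
  have htl := pv_tl_dig x h10
  have hmap := pv_tl_map x h10
  have hL := pv_tl_len x h10
  have hwin : (pvLastL ((PySem.Int.toChars x).map (fun c => ((c.toNat : Int) - 48))).length
      ([3, 7] : List Int)).map pvDC = ['3', '7'] := by
    have h37 : pvLastL ((PySem.Int.toChars x).map (fun c => ((c.toNat : Int) - 48))).length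
        ([3, 7] : List Int) = [3, 7] := by
      unfold pvLastL
      rw [show ([3, 7] : List Int).length
          - ((PySem.Int.toChars x).map (fun c => ((c.toNat : Int) - 48))).length = 0 by
        simp at hL ⊢
        omega]
      rfl
    rw [h37]
    decide
  have key := pv_A_char _ htl hL pvN 0 [3, 7] 0 1 rfl
    (by unfold pvN; norm_num) (by unfold pvN; norm_num)
  have hcs : ((#[3, 7] : Array Int).toList.map (fun c => PySem.Int.toChars c)).flatten
      = ['3', '7'] := by decide
  show pvA_loop (PySem.Int.toChars x) pvN (pvN - 2) #[3, 7] 0 1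
    ((#[3, 7] : Array Int).toList.map (fun c => PySem.Int.toChars c)).flatten
    ((#[3, 7] : Array Int).size : Int) = _
  rw [hcs]
  conv_lhs => rw [← hmap, ← hwin]
  exact key

lemma pv_B_eq (x : Int) (h10 : 10 ≤ x) :
    get_part_two_answer_alt x =
      pvAnsFrom ((PySem.Int.toChars x).map (fun c => ((c.toNat : Int) - 48)))
        ((PySem.Int.toChars x).map (fun c => ((c.toNat : Int) - 48))).length := by
  have key := pv_B_char _ (pv_tl_dig x h10) (pv_tl_len x h10) 51 32
    (by norm_num) (by unfold pvN; norm_num)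
  show pvB_loop (PySem.Int.toChars x) 51 32 = _
  conv_lhs => rw [← pv_tl_map x h10]
  exact key

lemma pv_full_take2 : pvFull.take 2 = [3, 7] := by
  rw [← pv_take_full 0 2 (by simp [pvS]) (by unfold pvN; norm_num)]
  rfl

lemma pv_main (x : Int) (h10 : 10 ≤ x) (hD : ¬ PySem.Int.toChars x = ['3', '7']) :
    get_part_two_answer x = get_part_two_answer_alt x := by
  rw [pv_A_eq x h10, pv_B_eq x h10]
  have hmap := pv_tl_map x h10
  have hL := pv_tl_len x h10
  rcases Nat.lt_or_ge ((PySem.Int.toChars x).map (fun c => ((c.toNat : Int) - 48))).length 3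
    with h3 | h3
  · -- a two-digit target: A skips only the never-checked end position 2,
    -- harmless unless the target is [3,7] itself (excluded by hD)
    have hL2 : ((PySem.Int.toChars x).map (fun c => ((c.toNat : Int) - 48))).length = 2 := by
      omega
    have hm2 : pvMatchEndB ((PySem.Int.toChars x).map (fun c => ((c.toNat : Int) - 48))) 2
        = false := by
      unfold pvMatchEndB
      rw [decide_eq_false_iff_not]
      intro hEq
      rw [pv_full_take2, hL2] at hEq
      have h37 : (PySem.Int.toChars x).map (fun c => ((c.toNat : Int) - 48)) = [3, 7] := by
        rw [← hEq]
        rfl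
      rw [h37] at hmap
      exact hD (by rw [← hmap]; rfl)
    rw [hL2]
    exact (pvAnsFrom_shift _ (by omega)
      (fun j hj1 hj2 => by rw [show j = 2 by omega]; exact hm2)).symm
  · exact pvAnsFrom_shift _ h3 (fun j hj1 hj2 => pv_matchEnd_small _ (by omega))
-- ---- witness evaluation at the intended-difference input 37 ----

lemma pv_mk37 : pvMake 32 32 #[3, 7] 0 1 = #[3, 7, 1, 0, 1, 0, 1, 2, 4, 5, 1, 5, 8, 9, 1, 6, 7, 7, 9, 2, 5, 1, 0, 7, 1, 0, 8, 5, 1, 0, 1, 1] := by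
  have m0 : pvMake 32 32 #[3, 7] 0 1 = pvMake 32 31 #[3, 7, 1, 0] 0 1 :=
    pvMake_step (by decide) (by decide) (by decide) (by decide)
  have m1 : pvMake 32 31 #[3, 7, 1, 0] 0 1 = pvMake 32 30 #[3, 7, 1, 0, 1, 0] 4 3 :=
    pvMake_step (by decide) (by decide) (by decide) (by decide)
  have m2 : pvMake 32 30 #[3, 7, 1, 0, 1, 0] 4 3 = pvMake 32 29 #[3, 7, 1, 0, 1, 0, 1] 6 4 :=
    pvMake_step (by decide) (by decide) (by decide) (by decide)
  have m3 : pvMake 32 29 #[3, 7, 1, 0, 1, 0, 1] 6 4 = pvMake 32 28 #[3, 7, 1, 0, 1, 0, 1, 2] 0 6 :=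
    pvMake_step (by decide) (by decide) (by decide) (by decide)
  have m4 : pvMake 32 28 #[3, 7, 1, 0, 1, 0, 1, 2] 0 6 = pvMake 32 27 #[3, 7, 1, 0, 1, 0, 1, 2, 4] 4 8 :=
    pvMake_step (by decide) (by decide) (by decide) (by decide)
  have m5 : pvMake 32 27 #[3, 7, 1, 0, 1, 0, 1, 2, 4] 4 8 = pvMake 32 26 #[3, 7, 1, 0, 1, 0, 1, 2, 4, 5] 6 3 :=
    pvMake_step (by decide) (by decide) (by decide) (by decide)
  have m6 : pvMake 32 26 #[3, 7, 1, 0, 1, 0, 1, 2, 4, 5] 6 3 = pvMake 32 25 #[3, 7, 1, 0, 1, 0, 1, 2, 4, 5, 1] 8 4 :=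
    pvMake_step (by decide) (by decide) (by decide) (by decide)
  have m7 : pvMake 32 25 #[3, 7, 1, 0, 1, 0, 1, 2, 4, 5, 1] 8 4 = pvMake 32 24 #[3, 7, 1, 0, 1, 0, 1, 2, 4, 5, 1, 5] 1 6 :=
    pvMake_step (by decide) (by decide) (by decide) (by decide)
  have m8 : pvMake 32 24 #[3, 7, 1, 0, 1, 0, 1, 2, 4, 5, 1, 5] 1 6 = pvMake 32 23 #[3, 7, 1, 0, 1, 0, 1, 2, 4, 5, 1, 5, 8] 9 8 :=
    pvMake_step (by decide) (by decide) (by decide) (by decide)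
  have m9 : pvMake 32 23 #[3, 7, 1, 0, 1, 0, 1, 2, 4, 5, 1, 5, 8] 9 8 = pvMake 32 22 #[3, 7, 1, 0, 1, 0, 1, 2, 4, 5, 1, 5, 8, 9] 1 13 :=
    pvMake_step (by decide) (by decide) (by decide) (by decide)
  have m10 : pvMake 32 22 #[3, 7, 1, 0, 1, 0, 1, 2, 4, 5, 1, 5, 8, 9] 1 13 = pvMake 32 21 #[3, 7, 1, 0, 1, 0, 1, 2, 4, 5, 1, 5, 8, 9, 1, 6] 9 7 :=
    pvMake_step (by decide) (by decide) (by decide) (by decide)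
  have m11 : pvMake 32 21 #[3, 7, 1, 0, 1, 0, 1, 2, 4, 5, 1, 5, 8, 9, 1, 6] 9 7 = pvMake 32 20 #[3, 7, 1, 0, 1, 0, 1, 2, 4, 5, 1, 5, 8, 9, 1, 6, 7] 15 10 :=
    pvMake_step (by decide) (by decide) (by decide) (by decide)
  have m12 : pvMake 32 20 #[3, 7, 1, 0, 1, 0, 1, 2, 4, 5, 1, 5, 8, 9, 1, 6, 7] 15 10 = pvMake 32 19 #[3, 7, 1, 0, 1, 0, 1, 2, 4, 5, 1, 5, 8, 9, 1, 6, 7, 7] 4 12 :=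
    pvMake_step (by decide) (by decide) (by decide) (by decide)
  have m13 : pvMake 32 19 #[3, 7, 1, 0, 1, 0, 1, 2, 4, 5, 1, 5, 8, 9, 1, 6, 7, 7] 4 12 = pvMake 32 18 #[3, 7, 1, 0, 1, 0, 1, 2, 4, 5, 1, 5, 8, 9, 1, 6, 7, 7, 9] 6 2 :=
    pvMake_step (by decide) (by decide) (by decide) (by decide)
  have m14 : pvMake 32 18 #[3, 7, 1, 0, 1, 0, 1, 2, 4, 5, 1, 5, 8, 9, 1, 6, 7, 7, 9] 6 2 = pvMake 32 17 #[3, 7, 1, 0, 1, 0, 1, 2, 4, 5, 1, 5, 8, 9, 1, 6, 7, 7, 9, 2] 8 4 :=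
    pvMake_step (by decide) (by decide) (by decide) (by decide)
  have m15 : pvMake 32 17 #[3, 7, 1, 0, 1, 0, 1, 2, 4, 5, 1, 5, 8, 9, 1, 6, 7, 7, 9, 2] 8 4 = pvMake 32 16 #[3, 7, 1, 0, 1, 0, 1, 2, 4, 5, 1, 5, 8, 9, 1, 6, 7, 7, 9, 2, 5] 13 6 :=
    pvMake_step (by decide) (by decide) (by decide) (by decide)
  have m16 : pvMake 32 16 #[3, 7, 1, 0, 1, 0, 1, 2, 4, 5, 1, 5, 8, 9, 1, 6, 7, 7, 9, 2, 5] 13 6 = pvMake 32 15 #[3, 7, 1, 0, 1, 0, 1, 2, 4, 5, 1, 5, 8, 9, 1, 6, 7, 7, 9, 2, 5, 1, 0] 0 8 :=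
    pvMake_step (by decide) (by decide) (by decide) (by decide)
  have m17 : pvMake 32 15 #[3, 7, 1, 0, 1, 0, 1, 2, 4, 5, 1, 5, 8, 9, 1, 6, 7, 7, 9, 2, 5, 1, 0] 0 8 = pvMake 32 14 #[3, 7, 1, 0, 1, 0, 1, 2, 4, 5, 1, 5, 8, 9, 1, 6, 7, 7, 9, 2, 5, 1, 0, 7] 4 13 :=
    pvMake_step (by decide) (by decide) (by decide) (by decide)
  have m18 : pvMake 32 14 #[3, 7, 1, 0, 1, 0, 1, 2, 4, 5, 1, 5, 8, 9, 1, 6, 7, 7, 9, 2, 5, 1, 0, 7] 4 13 = pvMake 32 13 #[3, 7, 1, 0, 1, 0, 1, 2, 4, 5, 1, 5, 8, 9, 1, 6, 7, 7, 9, 2, 5, 1, 0, 7, 1, 0] 6 23 :=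
    pvMake_step (by decide) (by decide) (by decide) (by decide)
  have m19 : pvMake 32 13 #[3, 7, 1, 0, 1, 0, 1, 2, 4, 5, 1, 5, 8, 9, 1, 6, 7, 7, 9, 2, 5, 1, 0, 7, 1, 0] 6 23 = pvMake 32 12 #[3, 7, 1, 0, 1, 0, 1, 2, 4, 5, 1, 5, 8, 9, 1, 6, 7, 7, 9, 2, 5, 1, 0, 7, 1, 0, 8] 8 4 :=
    pvMake_step (by decide) (by decide) (by decide) (by decide)
  have m20 : pvMake 32 12 #[3, 7, 1, 0, 1, 0, 1, 2, 4, 5, 1, 5, 8, 9, 1, 6, 7, 7, 9, 2, 5, 1, 0, 7, 1, 0, 8] 8 4 = pvMake 32 11 #[3, 7, 1, 0, 1, 0, 1, 2, 4, 5, 1, 5, 8, 9, 1, 6, 7, 7, 9, 2, 5, 1, 0, 7, 1, 0, 8, 5] 13 6 :=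
    pvMake_step (by decide) (by decide) (by decide) (by decide)
  have m21 : pvMake 32 11 #[3, 7, 1, 0, 1, 0, 1, 2, 4, 5, 1, 5, 8, 9, 1, 6, 7, 7, 9, 2, 5, 1, 0, 7, 1, 0, 8, 5] 13 6 = pvMake 32 10 #[3, 7, 1, 0, 1, 0, 1, 2, 4, 5, 1, 5, 8, 9, 1, 6, 7, 7, 9, 2, 5, 1, 0, 7, 1, 0, 8, 5, 1, 0] 23 8 :=
    pvMake_step (by decide) (by decide) (by decide) (by decide)
  have m22 : pvMake 32 10 #[3, 7, 1, 0, 1, 0, 1, 2, 4, 5, 1, 5, 8, 9, 1, 6, 7, 7, 9, 2, 5, 1, 0, 7, 1, 0, 8, 5, 1, 0] 23 8 = pvMake 32 9 #[3, 7, 1, 0, 1, 0, 1, 2, 4, 5, 1, 5, 8, 9, 1, 6, 7, 7, 9, 2, 5, 1, 0, 7, 1, 0, 8, 5, 1, 0, 1, 1] 31 13 :=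
    pvMake_step (by decide) (by decide) (by decide) (by decide)
  have mfin : pvMake 32 9 #[3, 7, 1, 0, 1, 0, 1, 2, 4, 5, 1, 5, 8, 9, 1, 6, 7, 7, 9, 2, 5, 1, 0, 7, 1, 0, 8, 5, 1, 0, 1, 1] 31 13 = #[3, 7, 1, 0, 1, 0, 1, 2, 4, 5, 1, 5, 8, 9, 1, 6, 7, 7, 9, 2, 5, 1, 0, 7, 1, 0, 8, 5, 1, 0, 1, 1] :=
    pvMake_stop' (by decide) _ (by decide)
  exact (((((((((((((((((((((((m0).trans m1).trans m2).trans m3).trans m4).trans m5).trans m6).trans m7).trans m8).trans m9).trans m10).trans m11).trans m12).trans m13).trans m14).trans m15).trans m16).trans m17).trans m18).trans m19).trans m20).trans m21).trans m22).trans mfin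

lemma pv_B_at_37 : get_part_two_answer_alt 37 = 0 := by
  have h0 : get_part_two_answer_alt 37 = pvB_loop ['3', '7'] 51 32 := by
    show pvB_loop (PySem.Int.toChars 37) 51 32 = _
    rw [show PySem.Int.toChars 37 = ['3', '7'] from by decide]
  rw [h0, show (51 : Nat) = 50 + 1 from rfl, pvB_loop_succ, pv_mk37]
  decide

set_option maxRecDepth 40000 in
set_option maxHeartbeats 8000000 in
lemma pv_A_at_37 : get_part_two_answer 37 = 145 := by
  have a_init : get_part_two_answer 37 = pvA_loop ['3', '7'] 36028797018963968 36028797018963966 #[3, 7] 0 1 ['3', '7'] 2 := by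
    show pvA_loop (PySem.Int.toChars 37) pvN (pvN - 2) #[3, 7] 0 1
      (((#[3, 7] : Array Int).toList.map (fun c => PySem.Int.toChars c)).flatten)
      ((#[3, 7] : Array Int).size : Int) = _
    rw [show PySem.Int.toChars 37 = ['3', '7'] from by decide,
      show (((#[3, 7] : Array Int).toList.map (fun c => PySem.Int.toChars c)).flatten)
        = ['3', '7'] from by decide,
      show ((#[3, 7] : Array Int).size : Int) = 2 from by decide]
    unfold pvN
    norm_num
  have a0 : pvA_loop ['3', '7'] 36028797018963968 36028797018963966 #[3, 7] 0 1 ['3', '7'] 2 = pvA_loop ['3', '7'] 36028797018963967 36028797018963964 #[3, 7, 1, 0] 0 1 ['1', '0'] 4 :=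
    pvA_step1 (by decide) (by decide) (by decide)
  have a1 : pvA_loop ['3', '7'] 36028797018963967 36028797018963964 #[3, 7, 1, 0] 0 1 ['1', '0'] 4 = pvA_loop ['3', '7'] 36028797018963966 36028797018963962 #[3, 7, 1, 0, 1, 0] 4 3 ['1', '0'] 6 :=
    pvA_step1 (by decide) (by decide) (by decide)
  have a2 : pvA_loop ['3', '7'] 36028797018963966 36028797018963962 #[3, 7, 1, 0, 1, 0] 4 3 ['1', '0'] 6 = pvA_loop ['3', '7'] 36028797018963965 36028797018963961 #[3, 7, 1, 0, 1, 0, 1] 6 4 ['0', '1'] 7 :=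
    pvA_step1 (by decide) (by decide) (by decide)
  have a3 : pvA_loop ['3', '7'] 36028797018963965 36028797018963961 #[3, 7, 1, 0, 1, 0, 1] 6 4 ['0', '1'] 7 = pvA_loop ['3', '7'] 36028797018963964 36028797018963960 #[3, 7, 1, 0, 1, 0, 1, 2] 0 6 ['1', '2'] 8 :=
    pvA_step1 (by decide) (by decide) (by decide)
  have a4 : pvA_loop ['3', '7'] 36028797018963964 36028797018963960 #[3, 7, 1, 0, 1, 0, 1, 2] 0 6 ['1', '2'] 8 = pvA_loop ['3', '7'] 36028797018963963 36028797018963959 #[3, 7, 1, 0, 1, 0, 1, 2, 4] 4 8 ['2', '4'] 9 :=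
    pvA_step1 (by decide) (by decide) (by decide)
  have a5 : pvA_loop ['3', '7'] 36028797018963963 36028797018963959 #[3, 7, 1, 0, 1, 0, 1, 2, 4] 4 8 ['2', '4'] 9 = pvA_loop ['3', '7'] 36028797018963962 36028797018963958 #[3, 7, 1, 0, 1, 0, 1, 2, 4, 5] 6 3 ['4', '5'] 10 :=
    pvA_step1 (by decide) (by decide) (by decide)
  have a6 : pvA_loop ['3', '7'] 36028797018963962 36028797018963958 #[3, 7, 1, 0, 1, 0, 1, 2, 4, 5] 6 3 ['4', '5'] 10 = pvA_loop ['3', '7'] 36028797018963961 36028797018963957 #[3, 7, 1, 0, 1, 0, 1, 2, 4, 5, 1] 8 4 ['5', '1'] 11 :=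
    pvA_step1 (by decide) (by decide) (by decide)
  have a7 : pvA_loop ['3', '7'] 36028797018963961 36028797018963957 #[3, 7, 1, 0, 1, 0, 1, 2, 4, 5, 1] 8 4 ['5', '1'] 11 = pvA_loop ['3', '7'] 36028797018963960 36028797018963956 #[3, 7, 1, 0, 1, 0, 1, 2, 4, 5, 1, 5] 1 6 ['1', '5'] 12 :=
    pvA_step1 (by decide) (by decide) (by decide)
  have a8 : pvA_loop ['3', '7'] 36028797018963960 36028797018963956 #[3, 7, 1, 0, 1, 0, 1, 2, 4, 5, 1, 5] 1 6 ['1', '5'] 12 = pvA_loop ['3', '7'] 36028797018963959 36028797018963955 #[3, 7, 1, 0, 1, 0, 1, 2, 4, 5, 1, 5, 8] 9 8 ['5', '8'] 13 :=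
    pvA_step1 (by decide) (by decide) (by decide)
  have a9 : pvA_loop ['3', '7'] 36028797018963959 36028797018963955 #[3, 7, 1, 0, 1, 0, 1, 2, 4, 5, 1, 5, 8] 9 8 ['5', '8'] 13 = pvA_loop ['3', '7'] 36028797018963958 36028797018963954 #[3, 7, 1, 0, 1, 0, 1, 2, 4, 5, 1, 5, 8, 9] 1 13 ['8', '9'] 14 :=
    pvA_step1 (by decide) (by decide) (by decide)
  have a10 : pvA_loop ['3', '7'] 36028797018963958 36028797018963954 #[3, 7, 1, 0, 1, 0, 1, 2, 4, 5, 1, 5, 8, 9] 1 13 ['8', '9'] 14 = pvA_loop ['3', '7'] 36028797018963957 36028797018963952 #[3, 7, 1, 0, 1, 0, 1, 2, 4, 5, 1, 5, 8, 9, 1, 6] 9 7 ['1', '6'] 16 :=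
    pvA_step1 (by decide) (by decide) (by decide)
  have a11 : pvA_loop ['3', '7'] 36028797018963957 36028797018963952 #[3, 7, 1, 0, 1, 0, 1, 2, 4, 5, 1, 5, 8, 9, 1, 6] 9 7 ['1', '6'] 16 = pvA_loop ['3', '7'] 36028797018963956 36028797018963951 #[3, 7, 1, 0, 1, 0, 1, 2, 4, 5, 1, 5, 8, 9, 1, 6, 7] 15 10 ['6', '7'] 17 :=
    pvA_step1 (by decide) (by decide) (by decide)
  have a12 : pvA_loop ['3', '7'] 36028797018963956 36028797018963951 #[3, 7, 1, 0, 1, 0, 1, 2, 4, 5, 1, 5, 8, 9, 1, 6, 7] 15 10 ['6', '7'] 17 = pvA_loop ['3', '7'] 36028797018963955 36028797018963950 #[3, 7, 1, 0, 1, 0, 1, 2, 4, 5, 1, 5, 8, 9, 1, 6, 7, 7] 4 12 ['7', '7'] 18 :=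
    pvA_step1 (by decide) (by decide) (by decide)
  have a13 : pvA_loop ['3', '7'] 36028797018963955 36028797018963950 #[3, 7, 1, 0, 1, 0, 1, 2, 4, 5, 1, 5, 8, 9, 1, 6, 7, 7] 4 12 ['7', '7'] 18 = pvA_loop ['3', '7'] 36028797018963954 36028797018963949 #[3, 7, 1, 0, 1, 0, 1, 2, 4, 5, 1, 5, 8, 9, 1, 6, 7, 7, 9] 6 2 ['7', '9'] 19 :=
    pvA_step1 (by decide) (by decide) (by decide)
  have a14 : pvA_loop ['3', '7'] 36028797018963954 36028797018963949 #[3, 7, 1, 0, 1, 0, 1, 2, 4, 5, 1, 5, 8, 9, 1, 6, 7, 7, 9] 6 2 ['7', '9'] 19 = pvA_loop ['3', '7'] 36028797018963953 36028797018963948 #[3, 7, 1, 0, 1, 0, 1, 2, 4, 5, 1, 5, 8, 9, 1, 6, 7, 7, 9, 2] 8 4 ['9', '2'] 20 :=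
    pvA_step1 (by decide) (by decide) (by decide)
  have a15 : pvA_loop ['3', '7'] 36028797018963953 36028797018963948 #[3, 7, 1, 0, 1, 0, 1, 2, 4, 5, 1, 5, 8, 9, 1, 6, 7, 7, 9, 2] 8 4 ['9', '2'] 20 = pvA_loop ['3', '7'] 36028797018963952 36028797018963947 #[3, 7, 1, 0, 1, 0, 1, 2, 4, 5, 1, 5, 8, 9, 1, 6, 7, 7, 9, 2, 5] 13 6 ['2', '5'] 21 :=
    pvA_step1 (by decide) (by decide) (by decide)
  have a16 : pvA_loop ['3', '7'] 36028797018963952 36028797018963947 #[3, 7, 1, 0, 1, 0, 1, 2, 4, 5, 1, 5, 8, 9, 1, 6, 7, 7, 9, 2, 5] 13 6 ['2', '5'] 21 = pvA_loop ['3', '7'] 36028797018963951 36028797018963945 #[3, 7, 1, 0, 1, 0, 1, 2, 4, 5, 1, 5, 8, 9, 1, 6, 7, 7, 9, 2, 5, 1, 0] 0 8 ['1', '0'] 23 :=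
    pvA_step1 (by decide) (by decide) (by decide)
  have a17 : pvA_loop ['3', '7'] 36028797018963951 36028797018963945 #[3, 7, 1, 0, 1, 0, 1, 2, 4, 5, 1, 5, 8, 9, 1, 6, 7, 7, 9, 2, 5, 1, 0] 0 8 ['1', '0'] 23 = pvA_loop ['3', '7'] 36028797018963950 36028797018963944 #[3, 7, 1, 0, 1, 0, 1, 2, 4, 5, 1, 5, 8, 9, 1, 6, 7, 7, 9, 2, 5, 1, 0, 7] 4 13 ['0', '7'] 24 :=
    pvA_step1 (by decide) (by decide) (by decide)
  have a18 : pvA_loop ['3', '7'] 36028797018963950 36028797018963944 #[3, 7, 1, 0, 1, 0, 1, 2, 4, 5, 1, 5, 8, 9, 1, 6, 7, 7, 9, 2, 5, 1, 0, 7] 4 13 ['0', '7'] 24 = pvA_loop ['3', '7'] 36028797018963949 36028797018963942 #[3, 7, 1, 0, 1, 0, 1, 2, 4, 5, 1, 5, 8, 9, 1, 6, 7, 7, 9, 2, 5, 1, 0, 7, 1, 0] 6 23 ['1', '0'] 26 :=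
    pvA_step1 (by decide) (by decide) (by decide)
  have a19 : pvA_loop ['3', '7'] 36028797018963949 36028797018963942 #[3, 7, 1, 0, 1, 0, 1, 2, 4, 5, 1, 5, 8, 9, 1, 6, 7, 7, 9, 2, 5, 1, 0, 7, 1, 0] 6 23 ['1', '0'] 26 = pvA_loop ['3', '7'] 36028797018963948 36028797018963941 #[3, 7, 1, 0, 1, 0, 1, 2, 4, 5, 1, 5, 8, 9, 1, 6, 7, 7, 9, 2, 5, 1, 0, 7, 1, 0, 8] 8 4 ['0', '8'] 27 :=
    pvA_step1 (by decide) (by decide) (by decide)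
  have a20 : pvA_loop ['3', '7'] 36028797018963948 36028797018963941 #[3, 7, 1, 0, 1, 0, 1, 2, 4, 5, 1, 5, 8, 9, 1, 6, 7, 7, 9, 2, 5, 1, 0, 7, 1, 0, 8] 8 4 ['0', '8'] 27 = pvA_loop ['3', '7'] 36028797018963947 36028797018963940 #[3, 7, 1, 0, 1, 0, 1, 2, 4, 5, 1, 5, 8, 9, 1, 6, 7, 7, 9, 2, 5, 1, 0, 7, 1, 0, 8, 5] 13 6 ['8', '5'] 28 :=
    pvA_step1 (by decide) (by decide) (by decide)
  have a21 : pvA_loop ['3', '7'] 36028797018963947 36028797018963940 #[3, 7, 1, 0, 1, 0, 1, 2, 4, 5, 1, 5, 8, 9, 1, 6, 7, 7, 9, 2, 5, 1, 0, 7, 1, 0, 8, 5] 13 6 ['8', '5'] 28 = pvA_loop ['3', '7'] 36028797018963946 36028797018963938 #[3, 7, 1, 0, 1, 0, 1, 2, 4, 5, 1, 5, 8, 9, 1, 6, 7, 7, 9, 2, 5, 1, 0, 7, 1, 0, 8, 5, 1, 0] 23 8 ['1', '0'] 30 :=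
    pvA_step1 (by decide) (by decide) (by decide)
  have a22 : pvA_loop ['3', '7'] 36028797018963946 36028797018963938 #[3, 7, 1, 0, 1, 0, 1, 2, 4, 5, 1, 5, 8, 9, 1, 6, 7, 7, 9, 2, 5, 1, 0, 7, 1, 0, 8, 5, 1, 0] 23 8 ['1', '0'] 30 = pvA_loop ['3', '7'] 36028797018963945 36028797018963936 #[3, 7, 1, 0, 1, 0, 1, 2, 4, 5, 1, 5, 8, 9, 1, 6, 7, 7, 9, 2, 5, 1, 0, 7, 1, 0, 8, 5, 1, 0, 1, 1] 31 13 ['1', '1'] 32 :=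
    pvA_step1 (by decide) (by decide) (by decide)
  have a23 : pvA_loop ['3', '7'] 36028797018963945 36028797018963936 #[3, 7, 1, 0, 1, 0, 1, 2, 4, 5, 1, 5, 8, 9, 1, 6, 7, 7, 9, 2, 5, 1, 0, 7, 1, 0, 8, 5, 1, 0, 1, 1] 31 13 ['1', '1'] 32 = pvA_loop ['3', '7'] 36028797018963944 36028797018963934 #[3, 7, 1, 0, 1, 0, 1, 2, 4, 5, 1, 5, 8, 9, 1, 6, 7, 7, 9, 2, 5, 1, 0, 7, 1, 0, 8, 5, 1, 0, 1, 1, 1, 0] 33 23 ['1', '0'] 34 :=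
    pvA_step1 (by decide) (by decide) (by decide)
  have a24 : pvA_loop ['3', '7'] 36028797018963944 36028797018963934 #[3, 7, 1, 0, 1, 0, 1, 2, 4, 5, 1, 5, 8, 9, 1, 6, 7, 7, 9, 2, 5, 1, 0, 7, 1, 0, 8, 5, 1, 0, 1, 1, 1, 0] 33 23 ['1', '0'] 34 = pvA_loop ['3', '7'] 36028797018963943 36028797018963933 #[3, 7, 1, 0, 1, 0, 1, 2, 4, 5, 1, 5, 8, 9, 1, 6, 7, 7, 9, 2, 5, 1, 0, 7, 1, 0, 8, 5, 1, 0, 1, 1, 1, 0, 7] 34 31 ['0', '7'] 35 :=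
    pvA_step1 (by decide) (by decide) (by decide)
  have a25 : pvA_loop ['3', '7'] 36028797018963943 36028797018963933 #[3, 7, 1, 0, 1, 0, 1, 2, 4, 5, 1, 5, 8, 9, 1, 6, 7, 7, 9, 2, 5, 1, 0, 7, 1, 0, 8, 5, 1, 0, 1, 1, 1, 0, 7] 34 31 ['0', '7'] 35 = pvA_loop ['3', '7'] 36028797018963942 36028797018963932 #[3, 7, 1, 0, 1, 0, 1, 2, 4, 5, 1, 5, 8, 9, 1, 6, 7, 7, 9, 2, 5, 1, 0, 7, 1, 0, 8, 5, 1, 0, 1, 1, 1, 0, 7, 8] 6 33 ['7', '8'] 36 :=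
    pvA_step1 (by decide) (by decide) (by decide)
  have a26 : pvA_loop ['3', '7'] 36028797018963942 36028797018963932 #[3, 7, 1, 0, 1, 0, 1, 2, 4, 5, 1, 5, 8, 9, 1, 6, 7, 7, 9, 2, 5, 1, 0, 7, 1, 0, 8, 5, 1, 0, 1, 1, 1, 0, 7, 8] 6 33 ['7', '8'] 36 = pvA_loop ['3', '7'] 36028797018963941 36028797018963931 #[3, 7, 1, 0, 1, 0, 1, 2, 4, 5, 1, 5, 8, 9, 1, 6, 7, 7, 9, 2, 5, 1, 0, 7, 1, 0, 8, 5, 1, 0, 1, 1, 1, 0, 7, 8, 1] 8 34 ['8', '1'] 37 :=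
    pvA_step1 (by decide) (by decide) (by decide)
  have a27 : pvA_loop ['3', '7'] 36028797018963941 36028797018963931 #[3, 7, 1, 0, 1, 0, 1, 2, 4, 5, 1, 5, 8, 9, 1, 6, 7, 7, 9, 2, 5, 1, 0, 7, 1, 0, 8, 5, 1, 0, 1, 1, 1, 0, 7, 8, 1] 8 34 ['8', '1'] 37 = pvA_loop ['3', '7'] 36028797018963940 36028797018963929 #[3, 7, 1, 0, 1, 0, 1, 2, 4, 5, 1, 5, 8, 9, 1, 6, 7, 7, 9, 2, 5, 1, 0, 7, 1, 0, 8, 5, 1, 0, 1, 1, 1, 0, 7, 8, 1, 1, 1] 13 3 ['1', '1'] 39 :=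
    pvA_step1 (by decide) (by decide) (by decide)
  have a28 : pvA_loop ['3', '7'] 36028797018963940 36028797018963929 #[3, 7, 1, 0, 1, 0, 1, 2, 4, 5, 1, 5, 8, 9, 1, 6, 7, 7, 9, 2, 5, 1, 0, 7, 1, 0, 8, 5, 1, 0, 1, 1, 1, 0, 7, 8, 1, 1, 1] 13 3 ['1', '1'] 39 = pvA_loop ['3', '7'] 36028797018963939 36028797018963928 #[3, 7, 1, 0, 1, 0, 1, 2, 4, 5, 1, 5, 8, 9, 1, 6, 7, 7, 9, 2, 5, 1, 0, 7, 1, 0, 8, 5, 1, 0, 1, 1, 1, 0, 7, 8, 1, 1, 1, 9] 23 4 ['1', '9'] 40 :=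
    pvA_step1 (by decide) (by decide) (by decide)
  have a29 : pvA_loop ['3', '7'] 36028797018963939 36028797018963928 #[3, 7, 1, 0, 1, 0, 1, 2, 4, 5, 1, 5, 8, 9, 1, 6, 7, 7, 9, 2, 5, 1, 0, 7, 1, 0, 8, 5, 1, 0, 1, 1, 1, 0, 7, 8, 1, 1, 1, 9] 23 4 ['1', '9'] 40 = pvA_loop ['3', '7'] 36028797018963938 36028797018963927 #[3, 7, 1, 0, 1, 0, 1, 2, 4, 5, 1, 5, 8, 9, 1, 6, 7, 7, 9, 2, 5, 1, 0, 7, 1, 0, 8, 5, 1, 0, 1, 1, 1, 0, 7, 8, 1, 1, 1, 9, 8] 31 6 ['9', '8'] 41 :=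
    pvA_step1 (by decide) (by decide) (by decide)
  have a30 : pvA_loop ['3', '7'] 36028797018963938 36028797018963927 #[3, 7, 1, 0, 1, 0, 1, 2, 4, 5, 1, 5, 8, 9, 1, 6, 7, 7, 9, 2, 5, 1, 0, 7, 1, 0, 8, 5, 1, 0, 1, 1, 1, 0, 7, 8, 1, 1, 1, 9, 8] 31 6 ['9', '8'] 41 = pvA_loop ['3', '7'] 36028797018963937 36028797018963926 #[3, 7, 1, 0, 1, 0, 1, 2, 4, 5, 1, 5, 8, 9, 1, 6, 7, 7, 9, 2, 5, 1, 0, 7, 1, 0, 8, 5, 1, 0, 1, 1, 1, 0, 7, 8, 1, 1, 1, 9, 8, 2] 33 8 ['8', '2'] 42 :=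
    pvA_step1 (by decide) (by decide) (by decide)
  have a31 : pvA_loop ['3', '7'] 36028797018963937 36028797018963926 #[3, 7, 1, 0, 1, 0, 1, 2, 4, 5, 1, 5, 8, 9, 1, 6, 7, 7, 9, 2, 5, 1, 0, 7, 1, 0, 8, 5, 1, 0, 1, 1, 1, 0, 7, 8, 1, 1, 1, 9, 8, 2] 33 8 ['8', '2'] 42 = pvA_loop ['3', '7'] 36028797018963936 36028797018963925 #[3, 7, 1, 0, 1, 0, 1, 2, 4, 5, 1, 5, 8, 9, 1, 6, 7, 7, 9, 2, 5, 1, 0, 7, 1, 0, 8, 5, 1, 0, 1, 1, 1, 0, 7, 8, 1, 1, 1, 9, 8, 2, 4] 34 13 ['2', '4'] 43 :=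
    pvA_step1 (by decide) (by decide) (by decide)
  have a32 : pvA_loop ['3', '7'] 36028797018963936 36028797018963925 #[3, 7, 1, 0, 1, 0, 1, 2, 4, 5, 1, 5, 8, 9, 1, 6, 7, 7, 9, 2, 5, 1, 0, 7, 1, 0, 8, 5, 1, 0, 1, 1, 1, 0, 7, 8, 1, 1, 1, 9, 8, 2, 4] 34 13 ['2', '4'] 43 = pvA_loop ['3', '7'] 36028797018963935 36028797018963923 #[3, 7, 1, 0, 1, 0, 1, 2, 4, 5, 1, 5, 8, 9, 1, 6, 7, 7, 9, 2, 5, 1, 0, 7, 1, 0, 8, 5, 1, 0, 1, 1, 1, 0, 7, 8, 1, 1, 1, 9, 8, 2, 4, 1, 6] 42 23 ['1', '6'] 45 :=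
    pvA_step1 (by decide) (by decide) (by decide)
  have a33 : pvA_loop ['3', '7'] 36028797018963935 36028797018963923 #[3, 7, 1, 0, 1, 0, 1, 2, 4, 5, 1, 5, 8, 9, 1, 6, 7, 7, 9, 2, 5, 1, 0, 7, 1, 0, 8, 5, 1, 0, 1, 1, 1, 0, 7, 8, 1, 1, 1, 9, 8, 2, 4, 1, 6] 42 23 ['1', '6'] 45 = pvA_loop ['3', '7'] 36028797018963934 36028797018963921 #[3, 7, 1, 0, 1, 0, 1, 2, 4, 5, 1, 5, 8, 9, 1, 6, 7, 7, 9, 2, 5, 1, 0, 7, 1, 0, 8, 5, 1, 0, 1, 1, 1, 0, 7, 8, 1, 1, 1, 9, 8, 2, 4, 1, 6, 1, 1] 0 31 ['1', '1'] 47 :=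
    pvA_step1 (by decide) (by decide) (by decide)
  have a34 : pvA_loop ['3', '7'] 36028797018963934 36028797018963921 #[3, 7, 1, 0, 1, 0, 1, 2, 4, 5, 1, 5, 8, 9, 1, 6, 7, 7, 9, 2, 5, 1, 0, 7, 1, 0, 8, 5, 1, 0, 1, 1, 1, 0, 7, 8, 1, 1, 1, 9, 8, 2, 4, 1, 6, 1, 1] 0 31 ['1', '1'] 47 = pvA_loop ['3', '7'] 36028797018963933 36028797018963920 #[3, 7, 1, 0, 1, 0, 1, 2, 4, 5, 1, 5, 8, 9, 1, 6, 7, 7, 9, 2, 5, 1, 0, 7, 1, 0, 8, 5, 1, 0, 1, 1, 1, 0, 7, 8, 1, 1, 1, 9, 8, 2, 4, 1, 6, 1, 1, 4] 4 33 ['1', '4'] 48 :=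
    pvA_step1 (by decide) (by decide) (by decide)
  have a35 : pvA_loop ['3', '7'] 36028797018963933 36028797018963920 #[3, 7, 1, 0, 1, 0, 1, 2, 4, 5, 1, 5, 8, 9, 1, 6, 7, 7, 9, 2, 5, 1, 0, 7, 1, 0, 8, 5, 1, 0, 1, 1, 1, 0, 7, 8, 1, 1, 1, 9, 8, 2, 4, 1, 6, 1, 1, 4] 4 33 ['1', '4'] 48 = pvA_loop ['3', '7'] 36028797018963932 36028797018963919 #[3, 7, 1, 0, 1, 0, 1, 2, 4, 5, 1, 5, 8, 9, 1, 6, 7, 7, 9, 2, 5, 1, 0, 7, 1, 0, 8, 5, 1, 0, 1, 1, 1, 0, 7, 8, 1, 1, 1, 9, 8, 2, 4, 1, 6, 1, 1, 4, 1] 6 34 ['4', '1'] 49 :=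
    pvA_step1 (by decide) (by decide) (by decide)
  have a36 : pvA_loop ['3', '7'] 36028797018963932 36028797018963919 #[3, 7, 1, 0, 1, 0, 1, 2, 4, 5, 1, 5, 8, 9, 1, 6, 7, 7, 9, 2, 5, 1, 0, 7, 1, 0, 8, 5, 1, 0, 1, 1, 1, 0, 7, 8, 1, 1, 1, 9, 8, 2, 4, 1, 6, 1, 1, 4, 1] 6 34 ['4', '1'] 49 = pvA_loop ['3', '7'] 36028797018963931 36028797018963918 #[3, 7, 1, 0, 1, 0, 1, 2, 4, 5, 1, 5, 8, 9, 1, 6, 7, 7, 9, 2, 5, 1, 0, 7, 1, 0, 8, 5, 1, 0, 1, 1, 1, 0, 7, 8, 1, 1, 1, 9, 8, 2, 4, 1, 6, 1, 1, 4, 1, 8] 8 42 ['1', '8'] 50 :=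
    pvA_step1 (by decide) (by decide) (by decide)
  have a37 : pvA_loop ['3', '7'] 36028797018963931 36028797018963918 #[3, 7, 1, 0, 1, 0, 1, 2, 4, 5, 1, 5, 8, 9, 1, 6, 7, 7, 9, 2, 5, 1, 0, 7, 1, 0, 8, 5, 1, 0, 1, 1, 1, 0, 7, 8, 1, 1, 1, 9, 8, 2, 4, 1, 6, 1, 1, 4, 1, 8] 8 42 ['1', '8'] 50 = pvA_loop ['3', '7'] 36028797018963930 36028797018963917 #[3, 7, 1, 0, 1, 0, 1, 2, 4, 5, 1, 5, 8, 9, 1, 6, 7, 7, 9, 2, 5, 1, 0, 7, 1, 0, 8, 5, 1, 0, 1, 1, 1, 0, 7, 8, 1, 1, 1, 9, 8, 2, 4, 1, 6, 1, 1, 4, 1, 8, 8] 13 47 ['8', '8'] 51 :=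
    pvA_step1 (by decide) (by decide) (by decide)
  have a38 : pvA_loop ['3', '7'] 36028797018963930 36028797018963917 #[3, 7, 1, 0, 1, 0, 1, 2, 4, 5, 1, 5, 8, 9, 1, 6, 7, 7, 9, 2, 5, 1, 0, 7, 1, 0, 8, 5, 1, 0, 1, 1, 1, 0, 7, 8, 1, 1, 1, 9, 8, 2, 4, 1, 6, 1, 1, 4, 1, 8, 8] 13 47 ['8', '8'] 51 = pvA_loop ['3', '7'] 36028797018963929 36028797018963915 #[3, 7, 1, 0, 1, 0, 1, 2, 4, 5, 1, 5, 8, 9, 1, 6, 7, 7, 9, 2, 5, 1, 0, 7, 1, 0, 8, 5, 1, 0, 1, 1, 1, 0, 7, 8, 1, 1, 1, 9, 8, 2, 4, 1, 6, 1, 1, 4, 1, 8, 8, 1, 3] 23 52 ['1', '3'] 53 :=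
    pvA_step1 (by decide) (by decide) (by decide)
  have a39 : pvA_loop ['3', '7'] 36028797018963929 36028797018963915 #[3, 7, 1, 0, 1, 0, 1, 2, 4, 5, 1, 5, 8, 9, 1, 6, 7, 7, 9, 2, 5, 1, 0, 7, 1, 0, 8, 5, 1, 0, 1, 1, 1, 0, 7, 8, 1, 1, 1, 9, 8, 2, 4, 1, 6, 1, 1, 4, 1, 8, 8, 1, 3] 23 52 ['1', '3'] 53 = pvA_loop ['3', '7'] 36028797018963928 36028797018963913 #[3, 7, 1, 0, 1, 0, 1, 2, 4, 5, 1, 5, 8, 9, 1, 6, 7, 7, 9, 2, 5, 1, 0, 7, 1, 0, 8, 5, 1, 0, 1, 1, 1, 0, 7, 8, 1, 1, 1, 9, 8, 2, 4, 1, 6, 1, 1, 4, 1, 8, 8, 1, 3, 1, 0] 31 1 ['1', '0'] 55 :=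
    pvA_step1 (by decide) (by decide) (by decide)
  have a40 : pvA_loop ['3', '7'] 36028797018963928 36028797018963913 #[3, 7, 1, 0, 1, 0, 1, 2, 4, 5, 1, 5, 8, 9, 1, 6, 7, 7, 9, 2, 5, 1, 0, 7, 1, 0, 8, 5, 1, 0, 1, 1, 1, 0, 7, 8, 1, 1, 1, 9, 8, 2, 4, 1, 6, 1, 1, 4, 1, 8, 8, 1, 3, 1, 0] 31 1 ['1', '0'] 55 = pvA_loop ['3', '7'] 36028797018963927 36028797018963912 #[3, 7, 1, 0, 1, 0, 1, 2, 4, 5, 1, 5, 8, 9, 1, 6, 7, 7, 9, 2, 5, 1, 0, 7, 1, 0, 8, 5, 1, 0, 1, 1, 1, 0, 7, 8, 1, 1, 1, 9, 8, 2, 4, 1, 6, 1, 1, 4, 1, 8, 8, 1, 3, 1, 0, 8] 33 9 ['0', '8'] 56 :=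
    pvA_step1 (by decide) (by decide) (by decide)
  have a41 : pvA_loop ['3', '7'] 36028797018963927 36028797018963912 #[3, 7, 1, 0, 1, 0, 1, 2, 4, 5, 1, 5, 8, 9, 1, 6, 7, 7, 9, 2, 5, 1, 0, 7, 1, 0, 8, 5, 1, 0, 1, 1, 1, 0, 7, 8, 1, 1, 1, 9, 8, 2, 4, 1, 6, 1, 1, 4, 1, 8, 8, 1, 3, 1, 0, 8] 33 9 ['0', '8'] 56 = pvA_loop ['3', '7'] 36028797018963926 36028797018963911 #[3, 7, 1, 0, 1, 0, 1, 2, 4, 5, 1, 5, 8, 9, 1, 6, 7, 7, 9, 2, 5, 1, 0, 7, 1, 0, 8, 5, 1, 0, 1, 1, 1, 0, 7, 8, 1, 1, 1, 9, 8, 2, 4, 1, 6, 1, 1, 4, 1, 8, 8, 1, 3, 1, 0, 8, 5] 34 15 ['8', '5'] 57 :=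
    pvA_step1 (by decide) (by decide) (by decide)
  have a42 : pvA_loop ['3', '7'] 36028797018963926 36028797018963911 #[3, 7, 1, 0, 1, 0, 1, 2, 4, 5, 1, 5, 8, 9, 1, 6, 7, 7, 9, 2, 5, 1, 0, 7, 1, 0, 8, 5, 1, 0, 1, 1, 1, 0, 7, 8, 1, 1, 1, 9, 8, 2, 4, 1, 6, 1, 1, 4, 1, 8, 8, 1, 3, 1, 0, 8, 5] 34 15 ['8', '5'] 57 = pvA_loop ['3', '7'] 36028797018963925 36028797018963909 #[3, 7, 1, 0, 1, 0, 1, 2, 4, 5, 1, 5, 8, 9, 1, 6, 7, 7, 9, 2, 5, 1, 0, 7, 1, 0, 8, 5, 1, 0, 1, 1, 1, 0, 7, 8, 1, 1, 1, 9, 8, 2, 4, 1, 6, 1, 1, 4, 1, 8, 8, 1, 3, 1, 0, 8, 5, 1, 3] 42 22 ['1', '3'] 59 :=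
    pvA_step1 (by decide) (by decide) (by decide)
  have a43 : pvA_loop ['3', '7'] 36028797018963925 36028797018963909 #[3, 7, 1, 0, 1, 0, 1, 2, 4, 5, 1, 5, 8, 9, 1, 6, 7, 7, 9, 2, 5, 1, 0, 7, 1, 0, 8, 5, 1, 0, 1, 1, 1, 0, 7, 8, 1, 1, 1, 9, 8, 2, 4, 1, 6, 1, 1, 4, 1, 8, 8, 1, 3, 1, 0, 8, 5, 1, 3] 42 22 ['1', '3'] 59 = pvA_loop ['3', '7'] 36028797018963924 36028797018963908 #[3, 7, 1, 0, 1, 0, 1, 2, 4, 5, 1, 5, 8, 9, 1, 6, 7, 7, 9, 2, 5, 1, 0, 7, 1, 0, 8, 5, 1, 0, 1, 1, 1, 0, 7, 8, 1, 1, 1, 9, 8, 2, 4, 1, 6, 1, 1, 4, 1, 8, 8, 1, 3, 1, 0, 8, 5, 1, 3, 4] 47 23 ['3', '4'] 60 :=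
    pvA_step1 (by decide) (by decide) (by decide)
  have a44 : pvA_loop ['3', '7'] 36028797018963924 36028797018963908 #[3, 7, 1, 0, 1, 0, 1, 2, 4, 5, 1, 5, 8, 9, 1, 6, 7, 7, 9, 2, 5, 1, 0, 7, 1, 0, 8, 5, 1, 0, 1, 1, 1, 0, 7, 8, 1, 1, 1, 9, 8, 2, 4, 1, 6, 1, 1, 4, 1, 8, 8, 1, 3, 1, 0, 8, 5, 1, 3, 4] 47 23 ['3', '4'] 60 = pvA_loop ['3', '7'] 36028797018963923 36028797018963906 #[3, 7, 1, 0, 1, 0, 1, 2, 4, 5, 1, 5, 8, 9, 1, 6, 7, 7, 9, 2, 5, 1, 0, 7, 1, 0, 8, 5, 1, 0, 1, 1, 1, 0, 7, 8, 1, 1, 1, 9, 8, 2, 4, 1, 6, 1, 1, 4, 1, 8, 8, 1, 3, 1, 0, 8, 5, 1, 3, 4, 1, 1] 52 31 ['1', '1'] 62 :=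
    pvA_step1 (by decide) (by decide) (by decide)
  have a45 : pvA_loop ['3', '7'] 36028797018963923 36028797018963906 #[3, 7, 1, 0, 1, 0, 1, 2, 4, 5, 1, 5, 8, 9, 1, 6, 7, 7, 9, 2, 5, 1, 0, 7, 1, 0, 8, 5, 1, 0, 1, 1, 1, 0, 7, 8, 1, 1, 1, 9, 8, 2, 4, 1, 6, 1, 1, 4, 1, 8, 8, 1, 3, 1, 0, 8, 5, 1, 3, 4, 1, 1] 52 31 ['1', '1'] 62 = pvA_loop ['3', '7'] 36028797018963922 36028797018963905 #[3, 7, 1, 0, 1, 0, 1, 2, 4, 5, 1, 5, 8, 9, 1, 6, 7, 7, 9, 2, 5, 1, 0, 7, 1, 0, 8, 5, 1, 0, 1, 1, 1, 0, 7, 8, 1, 1, 1, 9, 8, 2, 4, 1, 6, 1, 1, 4, 1, 8, 8, 1, 3, 1, 0, 8, 5, 1, 3, 4, 1, 1, 4] 56 33 ['1', '4'] 63 :=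
    pvA_step1 (by decide) (by decide) (by decide)
  have a46 : pvA_loop ['3', '7'] 36028797018963922 36028797018963905 #[3, 7, 1, 0, 1, 0, 1, 2, 4, 5, 1, 5, 8, 9, 1, 6, 7, 7, 9, 2, 5, 1, 0, 7, 1, 0, 8, 5, 1, 0, 1, 1, 1, 0, 7, 8, 1, 1, 1, 9, 8, 2, 4, 1, 6, 1, 1, 4, 1, 8, 8, 1, 3, 1, 0, 8, 5, 1, 3, 4, 1, 1, 4] 56 33 ['1', '4'] 63 = pvA_loop ['3', '7'] 36028797018963921 36028797018963904 #[3, 7, 1, 0, 1, 0, 1, 2, 4, 5, 1, 5, 8, 9, 1, 6, 7, 7, 9, 2, 5, 1, 0, 7, 1, 0, 8, 5, 1, 0, 1, 1, 1, 0, 7, 8, 1, 1, 1, 9, 8, 2, 4, 1, 6, 1, 1, 4, 1, 8, 8, 1, 3, 1, 0, 8, 5, 1, 3, 4, 1, 1, 4, 5] 62 34 ['4', '5'] 64 :=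
    pvA_step1 (by decide) (by decide) (by decide)
  have a47 : pvA_loop ['3', '7'] 36028797018963921 36028797018963904 #[3, 7, 1, 0, 1, 0, 1, 2, 4, 5, 1, 5, 8, 9, 1, 6, 7, 7, 9, 2, 5, 1, 0, 7, 1, 0, 8, 5, 1, 0, 1, 1, 1, 0, 7, 8, 1, 1, 1, 9, 8, 2, 4, 1, 6, 1, 1, 4, 1, 8, 8, 1, 3, 1, 0, 8, 5, 1, 3, 4, 1, 1, 4, 5] 62 34 ['4', '5'] 64 = pvA_loop ['3', '7'] 36028797018963920 36028797018963902 #[3, 7, 1, 0, 1, 0, 1, 2, 4, 5, 1, 5, 8, 9, 1, 6, 7, 7, 9, 2, 5, 1, 0, 7, 1, 0, 8, 5, 1, 0, 1, 1, 1, 0, 7, 8, 1, 1, 1, 9, 8, 2, 4, 1, 6, 1, 1, 4, 1, 8, 8, 1, 3, 1, 0, 8, 5, 1, 3, 4, 1, 1, 4, 5, 1, 1] 1 42 ['1', '1'] 66 :=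
    pvA_step1 (by decide) (by decide) (by decide)
  have a48 : pvA_loop ['3', '7'] 36028797018963920 36028797018963902 #[3, 7, 1, 0, 1, 0, 1, 2, 4, 5, 1, 5, 8, 9, 1, 6, 7, 7, 9, 2, 5, 1, 0, 7, 1, 0, 8, 5, 1, 0, 1, 1, 1, 0, 7, 8, 1, 1, 1, 9, 8, 2, 4, 1, 6, 1, 1, 4, 1, 8, 8, 1, 3, 1, 0, 8, 5, 1, 3, 4, 1, 1, 4, 5, 1, 1] 1 42 ['1', '1'] 66 = pvA_loop ['3', '7'] 36028797018963919 36028797018963900 #[3, 7, 1, 0, 1, 0, 1, 2, 4, 5, 1, 5, 8, 9, 1, 6, 7, 7, 9, 2, 5, 1, 0, 7, 1, 0, 8, 5, 1, 0, 1, 1, 1, 0, 7, 8, 1, 1, 1, 9, 8, 2, 4, 1, 6, 1, 1, 4, 1, 8, 8, 1, 3, 1, 0, 8, 5, 1, 3, 4, 1, 1, 4, 5, 1, 1, 1, 1] 9 47 ['1', '1'] 68 :=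
    pvA_step1 (by decide) (by decide) (by decide)
  have a49 : pvA_loop ['3', '7'] 36028797018963919 36028797018963900 #[3, 7, 1, 0, 1, 0, 1, 2, 4, 5, 1, 5, 8, 9, 1, 6, 7, 7, 9, 2, 5, 1, 0, 7, 1, 0, 8, 5, 1, 0, 1, 1, 1, 0, 7, 8, 1, 1, 1, 9, 8, 2, 4, 1, 6, 1, 1, 4, 1, 8, 8, 1, 3, 1, 0, 8, 5, 1, 3, 4, 1, 1, 4, 5, 1, 1, 1, 1] 9 47 ['1', '1'] 68 = pvA_loop ['3', '7'] 36028797018963918 36028797018963899 #[3, 7, 1, 0, 1, 0, 1, 2, 4, 5, 1, 5, 8, 9, 1, 6, 7, 7, 9, 2, 5, 1, 0, 7, 1, 0, 8, 5, 1, 0, 1, 1, 1, 0, 7, 8, 1, 1, 1, 9, 8, 2, 4, 1, 6, 1, 1, 4, 1, 8, 8, 1, 3, 1, 0, 8, 5, 1, 3, 4, 1, 1, 4, 5, 1, 1, 1, 1, 9] 15 52 ['1', '9'] 69 :=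
    pvA_step1 (by decide) (by decide) (by decide)
  have a50 : pvA_loop ['3', '7'] 36028797018963918 36028797018963899 #[3, 7, 1, 0, 1, 0, 1, 2, 4, 5, 1, 5, 8, 9, 1, 6, 7, 7, 9, 2, 5, 1, 0, 7, 1, 0, 8, 5, 1, 0, 1, 1, 1, 0, 7, 8, 1, 1, 1, 9, 8, 2, 4, 1, 6, 1, 1, 4, 1, 8, 8, 1, 3, 1, 0, 8, 5, 1, 3, 4, 1, 1, 4, 5, 1, 1, 1, 1, 9] 15 52 ['1', '9'] 69 = pvA_loop ['3', '7'] 36028797018963917 36028797018963898 #[3, 7, 1, 0, 1, 0, 1, 2, 4, 5, 1, 5, 8, 9, 1, 6, 7, 7, 9, 2, 5, 1, 0, 7, 1, 0, 8, 5, 1, 0, 1, 1, 1, 0, 7, 8, 1, 1, 1, 9, 8, 2, 4, 1, 6, 1, 1, 4, 1, 8, 8, 1, 3, 1, 0, 8, 5, 1, 3, 4, 1, 1, 4, 5, 1, 1, 1, 1, 9, 9] 22 56 ['9', '9'] 70 :=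
    pvA_step1 (by decide) (by decide) (by decide)
  have a51 : pvA_loop ['3', '7'] 36028797018963917 36028797018963898 #[3, 7, 1, 0, 1, 0, 1, 2, 4, 5, 1, 5, 8, 9, 1, 6, 7, 7, 9, 2, 5, 1, 0, 7, 1, 0, 8, 5, 1, 0, 1, 1, 1, 0, 7, 8, 1, 1, 1, 9, 8, 2, 4, 1, 6, 1, 1, 4, 1, 8, 8, 1, 3, 1, 0, 8, 5, 1, 3, 4, 1, 1, 4, 5, 1, 1, 1, 1, 9, 9] 22 56 ['9', '9'] 70 = pvA_loop ['3', '7'] 36028797018963916 36028797018963897 #[3, 7, 1, 0, 1, 0, 1, 2, 4, 5, 1, 5, 8, 9, 1, 6, 7, 7, 9, 2, 5, 1, 0, 7, 1, 0, 8, 5, 1, 0, 1, 1, 1, 0, 7, 8, 1, 1, 1, 9, 8, 2, 4, 1, 6, 1, 1, 4, 1, 8, 8, 1, 3, 1, 0, 8, 5, 1, 3, 4, 1, 1, 4, 5, 1, 1, 1, 1, 9, 9, 5] 23 62 ['9', '5'] 71 :=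
    pvA_step1 (by decide) (by decide) (by decide)
  have a52 : pvA_loop ['3', '7'] 36028797018963916 36028797018963897 #[3, 7, 1, 0, 1, 0, 1, 2, 4, 5, 1, 5, 8, 9, 1, 6, 7, 7, 9, 2, 5, 1, 0, 7, 1, 0, 8, 5, 1, 0, 1, 1, 1, 0, 7, 8, 1, 1, 1, 9, 8, 2, 4, 1, 6, 1, 1, 4, 1, 8, 8, 1, 3, 1, 0, 8, 5, 1, 3, 4, 1, 1, 4, 5, 1, 1, 1, 1, 9, 9, 5] 23 62 ['9', '5'] 71 = pvA_loop ['3', '7'] 36028797018963915 36028797018963895 #[3, 7, 1, 0, 1, 0, 1, 2, 4, 5, 1, 5, 8, 9, 1, 6, 7, 7, 9, 2, 5, 1, 0, 7, 1, 0, 8, 5, 1, 0, 1, 1, 1, 0, 7, 8, 1, 1, 1, 9, 8, 2, 4, 1, 6, 1, 1, 4, 1, 8, 8, 1, 3, 1, 0, 8, 5, 1, 3, 4, 1, 1, 4, 5, 1, 1, 1, 1, 9, 9, 5, 1, 1] 31 67 ['1', '1'] 73 :=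
    pvA_step1 (by decide) (by decide) (by decide)
  have a53 : pvA_loop ['3', '7'] 36028797018963915 36028797018963895 #[3, 7, 1, 0, 1, 0, 1, 2, 4, 5, 1, 5, 8, 9, 1, 6, 7, 7, 9, 2, 5, 1, 0, 7, 1, 0, 8, 5, 1, 0, 1, 1, 1, 0, 7, 8, 1, 1, 1, 9, 8, 2, 4, 1, 6, 1, 1, 4, 1, 8, 8, 1, 3, 1, 0, 8, 5, 1, 3, 4, 1, 1, 4, 5, 1, 1, 1, 1, 9, 9, 5, 1, 1] 31 67 ['1', '1'] 73 = pvA_loop ['3', '7'] 36028797018963914 36028797018963894 #[3, 7, 1, 0, 1, 0, 1, 2, 4, 5, 1, 5, 8, 9, 1, 6, 7, 7, 9, 2, 5, 1, 0, 7, 1, 0, 8, 5, 1, 0, 1, 1, 1, 0, 7, 8, 1, 1, 1, 9, 8, 2, 4, 1, 6, 1, 1, 4, 1, 8, 8, 1, 3, 1, 0, 8, 5, 1, 3, 4, 1, 1, 4, 5, 1, 1, 1, 1, 9, 9, 5, 1, 1, 2] 33 69 ['1', '2'] 74 :=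
    pvA_step1 (by decide) (by decide) (by decide)
  have a54 : pvA_loop ['3', '7'] 36028797018963914 36028797018963894 #[3, 7, 1, 0, 1, 0, 1, 2, 4, 5, 1, 5, 8, 9, 1, 6, 7, 7, 9, 2, 5, 1, 0, 7, 1, 0, 8, 5, 1, 0, 1, 1, 1, 0, 7, 8, 1, 1, 1, 9, 8, 2, 4, 1, 6, 1, 1, 4, 1, 8, 8, 1, 3, 1, 0, 8, 5, 1, 3, 4, 1, 1, 4, 5, 1, 1, 1, 1, 9, 9, 5, 1, 1, 2] 33 69 ['1', '2'] 74 = pvA_loop ['3', '7'] 36028797018963913 36028797018963893 #[3, 7, 1, 0, 1, 0, 1, 2, 4, 5, 1, 5, 8, 9, 1, 6, 7, 7, 9, 2, 5, 1, 0, 7, 1, 0, 8, 5, 1, 0, 1, 1, 1, 0, 7, 8, 1, 1, 1, 9, 8, 2, 4, 1, 6, 1, 1, 4, 1, 8, 8, 1, 3, 1, 0, 8, 5, 1, 3, 4, 1, 1, 4, 5, 1, 1, 1, 1, 9, 9, 5, 1, 1, 2, 9] 34 4 ['2', '9'] 75 :=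
    pvA_step1 (by decide) (by decide) (by decide)
  have a55 : pvA_loop ['3', '7'] 36028797018963913 36028797018963893 #[3, 7, 1, 0, 1, 0, 1, 2, 4, 5, 1, 5, 8, 9, 1, 6, 7, 7, 9, 2, 5, 1, 0, 7, 1, 0, 8, 5, 1, 0, 1, 1, 1, 0, 7, 8, 1, 1, 1, 9, 8, 2, 4, 1, 6, 1, 1, 4, 1, 8, 8, 1, 3, 1, 0, 8, 5, 1, 3, 4, 1, 1, 4, 5, 1, 1, 1, 1, 9, 9, 5, 1, 1, 2, 9] 34 4 ['2', '9'] 75 = pvA_loop ['3', '7'] 36028797018963912 36028797018963892 #[3, 7, 1, 0, 1, 0, 1, 2, 4, 5, 1, 5, 8, 9, 1, 6, 7, 7, 9, 2, 5, 1, 0, 7, 1, 0, 8, 5, 1, 0, 1, 1, 1, 0, 7, 8, 1, 1, 1, 9, 8, 2, 4, 1, 6, 1, 1, 4, 1, 8, 8, 1, 3, 1, 0, 8, 5, 1, 3, 4, 1, 1, 4, 5, 1, 1, 1, 1, 9, 9, 5, 1, 1, 2, 9, 8] 42 6 ['9', '8'] 76 :=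
    pvA_step1 (by decide) (by decide) (by decide)
  have a56 : pvA_loop ['3', '7'] 36028797018963912 36028797018963892 #[3, 7, 1, 0, 1, 0, 1, 2, 4, 5, 1, 5, 8, 9, 1, 6, 7, 7, 9, 2, 5, 1, 0, 7, 1, 0, 8, 5, 1, 0, 1, 1, 1, 0, 7, 8, 1, 1, 1, 9, 8, 2, 4, 1, 6, 1, 1, 4, 1, 8, 8, 1, 3, 1, 0, 8, 5, 1, 3, 4, 1, 1, 4, 5, 1, 1, 1, 1, 9, 9, 5, 1, 1, 2, 9, 8] 42 6 ['9', '8'] 76 = pvA_loop ['3', '7'] 36028797018963911 36028797018963891 #[3, 7, 1, 0, 1, 0, 1, 2, 4, 5, 1, 5, 8, 9, 1, 6, 7, 7, 9, 2, 5, 1, 0, 7, 1, 0, 8, 5, 1, 0, 1, 1, 1, 0, 7, 8, 1, 1, 1, 9, 8, 2, 4, 1, 6, 1, 1, 4, 1, 8, 8, 1, 3, 1, 0, 8, 5, 1, 3, 4, 1, 1, 4, 5, 1, 1, 1, 1, 9, 9, 5, 1, 1, 2, 9, 8, 5] 47 8 ['8', '5'] 77 :=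
    pvA_step1 (by decide) (by decide) (by decide)
  have a57 : pvA_loop ['3', '7'] 36028797018963911 36028797018963891 #[3, 7, 1, 0, 1, 0, 1, 2, 4, 5, 1, 5, 8, 9, 1, 6, 7, 7, 9, 2, 5, 1, 0, 7, 1, 0, 8, 5, 1, 0, 1, 1, 1, 0, 7, 8, 1, 1, 1, 9, 8, 2, 4, 1, 6, 1, 1, 4, 1, 8, 8, 1, 3, 1, 0, 8, 5, 1, 3, 4, 1, 1, 4, 5, 1, 1, 1, 1, 9, 9, 5, 1, 1, 2, 9, 8, 5] 47 8 ['8', '5'] 77 = pvA_loop ['3', '7'] 36028797018963910 36028797018963890 #[3, 7, 1, 0, 1, 0, 1, 2, 4, 5, 1, 5, 8, 9, 1, 6, 7, 7, 9, 2, 5, 1, 0, 7, 1, 0, 8, 5, 1, 0, 1, 1, 1, 0, 7, 8, 1, 1, 1, 9, 8, 2, 4, 1, 6, 1, 1, 4, 1, 8, 8, 1, 3, 1, 0, 8, 5, 1, 3, 4, 1, 1, 4, 5, 1, 1, 1, 1, 9, 9, 5, 1, 1, 2, 9, 8, 5, 8] 52 13 ['5', '8'] 78 :=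
    pvA_step1 (by decide) (by decide) (by decide)
  have a58 : pvA_loop ['3', '7'] 36028797018963910 36028797018963890 #[3, 7, 1, 0, 1, 0, 1, 2, 4, 5, 1, 5, 8, 9, 1, 6, 7, 7, 9, 2, 5, 1, 0, 7, 1, 0, 8, 5, 1, 0, 1, 1, 1, 0, 7, 8, 1, 1, 1, 9, 8, 2, 4, 1, 6, 1, 1, 4, 1, 8, 8, 1, 3, 1, 0, 8, 5, 1, 3, 4, 1, 1, 4, 5, 1, 1, 1, 1, 9, 9, 5, 1, 1, 2, 9, 8, 5, 8] 52 13 ['5', '8'] 78 = pvA_loop ['3', '7'] 36028797018963909 36028797018963888 #[3, 7, 1, 0, 1, 0, 1, 2, 4, 5, 1, 5, 8, 9, 1, 6, 7, 7, 9, 2, 5, 1, 0, 7, 1, 0, 8, 5, 1, 0, 1, 1, 1, 0, 7, 8, 1, 1, 1, 9, 8, 2, 4, 1, 6, 1, 1, 4, 1, 8, 8, 1, 3, 1, 0, 8, 5, 1, 3, 4, 1, 1, 4, 5, 1, 1, 1, 1, 9, 9, 5, 1, 1, 2, 9, 8, 5, 8, 1, 2] 56 23 ['1', '2'] 80 :=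
    pvA_step1 (by decide) (by decide) (by decide)
  have a59 : pvA_loop ['3', '7'] 36028797018963909 36028797018963888 #[3, 7, 1, 0, 1, 0, 1, 2, 4, 5, 1, 5, 8, 9, 1, 6, 7, 7, 9, 2, 5, 1, 0, 7, 1, 0, 8, 5, 1, 0, 1, 1, 1, 0, 7, 8, 1, 1, 1, 9, 8, 2, 4, 1, 6, 1, 1, 4, 1, 8, 8, 1, 3, 1, 0, 8, 5, 1, 3, 4, 1, 1, 4, 5, 1, 1, 1, 1, 9, 9, 5, 1, 1, 2, 9, 8, 5, 8, 1, 2] 56 23 ['1', '2'] 80 = pvA_loop ['3', '7'] 36028797018963908 36028797018963886 #[3, 7, 1, 0, 1, 0, 1, 2, 4, 5, 1, 5, 8, 9, 1, 6, 7, 7, 9, 2, 5, 1, 0, 7, 1, 0, 8, 5, 1, 0, 1, 1, 1, 0, 7, 8, 1, 1, 1, 9, 8, 2, 4, 1, 6, 1, 1, 4, 1, 8, 8, 1, 3, 1, 0, 8, 5, 1, 3, 4, 1, 1, 4, 5, 1, 1, 1, 1, 9, 9, 5, 1, 1, 2, 9, 8, 5, 8, 1, 2, 1, 2] 62 31 ['1',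 '2'] 82 :=
    pvA_step1 (by decide) (by decide) (by decide)
  have a60 : pvA_loop ['3', '7'] 36028797018963908 36028797018963886 #[3, 7, 1, 0, 1, 0, 1, 2, 4, 5, 1, 5, 8, 9, 1, 6, 7, 7, 9, 2, 5, 1, 0, 7, 1, 0, 8, 5, 1, 0, 1, 1, 1, 0, 7, 8, 1, 1, 1, 9, 8, 2, 4, 1, 6, 1, 1, 4, 1, 8, 8, 1, 3, 1, 0, 8, 5, 1, 3, 4, 1, 1, 4, 5, 1, 1, 1, 1, 9, 9, 5, 1, 1, 2, 9, 8, 5, 8, 1, 2, 1, 2] 62 31 ['1', '2'] 82 = pvA_loop ['3', '7'] 36028797018963907 36028797018963885 #[3, 7, 1, 0, 1, 0, 1, 2, 4, 5, 1, 5, 8, 9, 1, 6, 7, 7, 9, 2, 5, 1, 0, 7, 1, 0, 8, 5, 1, 0, 1, 1, 1, 0, 7, 8, 1, 1, 1, 9, 8, 2, 4, 1, 6, 1, 1, 4, 1, 8, 8, 1, 3, 1, 0, 8, 5, 1, 3, 4, 1, 1, 4, 5, 1, 1, 1, 1, 9, 9, 5, 1, 1, 2, 9, 8, 5, 8, 1,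 2, 1, 2, 5] 67 33 ['2', '5'] 83 :=
    pvA_step1 (by decide) (by decide) (by decide)
  have a61 : pvA_loop ['3', '7'] 36028797018963907 36028797018963885 #[3, 7, 1, 0, 1, 0, 1, 2, 4, 5, 1, 5, 8, 9, 1, 6, 7, 7, 9, 2, 5, 1, 0, 7, 1, 0, 8, 5, 1, 0, 1, 1, 1, 0, 7, 8, 1, 1, 1, 9, 8, 2, 4, 1, 6, 1, 1, 4, 1, 8, 8, 1, 3, 1, 0, 8, 5, 1, 3, 4, 1, 1, 4, 5, 1, 1, 1, 1, 9, 9, 5, 1, 1, 2, 9, 8, 5, 8, 1, 2, 1, 2, 5] 67 33 ['2', '5'] 83 = pvA_loop ['3', '7'] 36028797018963906 36028797018963884 #[3, 7, 1, 0, 1, 0, 1, 2, 4, 5, 1, 5, 8, 9, 1, 6, 7, 7, 9, 2, 5, 1, 0, 7, 1, 0, 8, 5, 1, 0, 1, 1, 1, 0, 7, 8, 1, 1, 1, 9, 8, 2, 4, 1, 6, 1, 1, 4, 1, 8, 8, 1, 3, 1, 0, 8, 5, 1, 3, 4, 1, 1, 4, 5, 1, 1, 1, 1, 9, 9, 5,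 1, 1, 2, 9, 8, 5, 8, 1, 2, 1, 2, 5, 1] 69 34 ['5', '1'] 84 :=
    pvA_step1 (by decide) (by decide) (by decide)
  have a62 : pvA_loop ['3', '7'] 36028797018963906 36028797018963884 #[3, 7, 1, 0, 1, 0, 1, 2, 4, 5, 1, 5, 8, 9, 1, 6, 7, 7, 9, 2, 5, 1, 0, 7, 1, 0, 8, 5, 1, 0, 1, 1, 1, 0, 7, 8, 1, 1, 1, 9, 8, 2, 4, 1, 6, 1, 1, 4, 1, 8, 8, 1, 3, 1, 0, 8, 5, 1, 3, 4, 1, 1, 4, 5, 1, 1, 1, 1, 9, 9, 5, 1, 1, 2, 9, 8, 5, 8, 1, 2, 1, 2, 5, 1] 69 34 ['5', '1'] 84 = pvA_loop ['3', '7'] 36028797018963905 36028797018963882 #[3, 7, 1, 0, 1, 0, 1, 2, 4, 5, 1, 5, 8, 9, 1, 6, 7, 7, 9, 2, 5, 1, 0, 7, 1, 0, 8, 5, 1, 0, 1, 1, 1, 0, 7, 8, 1, 1, 1, 9, 8, 2, 4, 1, 6, 1, 1, 4, 1, 8, 8, 1, 3, 1, 0, 8, 5, 1, 3, 4, 1,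 1, 4, 5, 1, 1, 1, 1, 9, 9, 5, 1, 1, 2, 9, 8, 5, 8, 1, 2, 1, 2, 5, 1, 1, 6] 79 42 ['1', '6'] 86 :=
    pvA_step1 (by decide) (by decide) (by decide)
  have a63 : pvA_loop ['3', '7'] 36028797018963905 36028797018963882 #[3, 7, 1, 0, 1, 0, 1, 2, 4, 5, 1, 5, 8, 9, 1, 6, 7, 7, 9, 2, 5, 1, 0, 7, 1, 0, 8, 5, 1, 0, 1, 1, 1, 0, 7, 8, 1, 1, 1, 9, 8, 2, 4, 1, 6, 1, 1, 4, 1, 8, 8, 1, 3, 1, 0, 8, 5, 1, 3, 4, 1, 1, 4, 5, 1, 1, 1, 1, 9, 9, 5, 1, 1, 2, 9, 8, 5, 8, 1, 2, 1, 2, 5, 1, 1, 6] 79 42 ['1', '6'] 86 = pvA_loop ['3', '7'] 36028797018963904 36028797018963881 #[3, 7, 1, 0, 1, 0, 1, 2, 4, 5, 1, 5, 8, 9, 1, 6, 7, 7, 9, 2, 5, 1, 0, 7, 1, 0, 8, 5, 1, 0, 1, 1, 1, 0, 7, 8, 1, 1, 1, 9, 8, 2, 4, 1, 6, 1, 1,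 4, 1, 8, 8, 1, 3, 1, 0, 8, 5, 1, 3, 4, 1, 1, 4, 5, 1, 1, 1, 1, 9, 9, 5, 1, 1, 2, 9, 8, 5, 8, 1, 2, 1, 2, 5, 1, 1, 6, 6] 82 47 ['6', '6'] 87 :=
    pvA_step1 (by decide) (by decide) (by decide)
  have a64 : pvA_loop ['3', '7'] 36028797018963904 36028797018963881 #[3, 7, 1, 0, 1, 0, 1, 2, 4, 5, 1, 5, 8, 9, 1, 6, 7, 7, 9, 2, 5, 1, 0, 7, 1, 0, 8, 5, 1, 0, 1, 1, 1, 0, 7, 8, 1, 1, 1, 9, 8, 2, 4, 1, 6, 1, 1, 4, 1, 8, 8, 1, 3, 1, 0, 8, 5, 1, 3, 4, 1, 1, 4, 5, 1, 1, 1, 1, 9, 9, 5, 1, 1, 2, 9, 8, 5, 8, 1, 2, 1, 2, 5, 1, 1, 6, 6] 82 47 ['6', '6'] 87 = pvA_loop ['3', '7'] 36028797018963903 36028797018963880 #[3, 7, 1, 0, 1, 0, 1, 2, 4, 5, 1, 5, 8, 9, 1, 6, 7, 7, 9, 2, 5, 1, 0, 7, 1, 0, 8, 5, 1, 0, 1,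 1, 1, 0, 7, 8, 1, 1, 1, 9, 8, 2, 4, 1, 6, 1, 1, 4, 1, 8, 8, 1, 3, 1, 0, 8, 5, 1, 3, 4, 1, 1, 4, 5, 1, 1, 1, 1, 9, 9, 5, 1, 1, 2, 9, 8, 5, 8, 1, 2, 1, 2, 5, 1, 1, 6, 6, 9] 0 52 ['6', '9'] 88 :=
    pvA_step1 (by decide) (by decide) (by decide)
  have a65 : pvA_loop ['3', '7'] 36028797018963903 36028797018963880 #[3, 7, 1, 0, 1, 0, 1, 2, 4, 5, 1, 5, 8, 9, 1, 6, 7, 7, 9, 2, 5, 1, 0, 7, 1, 0, 8, 5, 1, 0, 1, 1, 1, 0, 7, 8, 1, 1, 1, 9, 8, 2, 4, 1, 6, 1, 1, 4, 1, 8, 8, 1, 3, 1, 0, 8, 5, 1, 3, 4, 1, 1, 4, 5, 1, 1, 1, 1, 9, 9, 5, 1, 1, 2, 9, 8, 5, 8, 1, 2, 1, 2, 5, 1, 1, 6, 6, 9] 0 52 ['6', '9'] 88 = pvA_loop ['3', '7'] 36028797018963902 36028797018963879 #[3, 7, 1, 0, 1, 0, 1, 2, 4, 5, 1, 5, 8,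 9, 1, 6, 7, 7, 9, 2, 5, 1, 0, 7, 1, 0, 8, 5, 1, 0, 1, 1, 1, 0, 7, 8, 1, 1, 1, 9, 8, 2, 4, 1, 6, 1, 1, 4, 1, 8, 8, 1, 3, 1, 0, 8, 5, 1, 3, 4, 1, 1, 4, 5, 1, 1, 1, 1, 9, 9, 5, 1, 1, 2, 9, 8, 5, 8, 1, 2, 1, 2, 5, 1, 1, 6, 6, 9, 6] 4 56 ['9', '6'] 89 :=
    pvA_step1 (by decide) (by decide) (by decide)
  have a66 : pvA_loop ['3', '7'] 36028797018963902 36028797018963879 #[3, 7, 1, 0, 1, 0, 1, 2, 4, 5, 1, 5, 8, 9, 1, 6, 7, 7, 9, 2, 5, 1, 0, 7, 1, 0, 8, 5, 1, 0, 1, 1, 1, 0, 7, 8, 1, 1, 1, 9, 8, 2, 4, 1, 6, 1, 1, 4, 1, 8, 8, 1, 3, 1, 0, 8, 5, 1, 3, 4, 1, 1, 4, 5, 1, 1, 1, 1, 9, 9, 5, 1, 1, 2, 9, 8, 5, 8, 1, 2, 1, 2, 5, 1, 1, 6, 6, 9, 6] 4 56 ['9', '6'] 89 = pvA_loop ['3',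 '7'] 36028797018963901 36028797018963878 #[3, 7, 1, 0, 1, 0, 1, 2, 4, 5, 1, 5, 8, 9, 1, 6, 7, 7, 9, 2, 5, 1, 0, 7, 1, 0, 8, 5, 1, 0, 1, 1, 1, 0, 7, 8, 1, 1, 1, 9, 8, 2, 4, 1, 6, 1, 1, 4, 1, 8, 8, 1, 3, 1, 0, 8, 5, 1, 3, 4, 1, 1, 4, 5, 1, 1, 1, 1, 9, 9, 5, 1, 1, 2, 9, 8, 5, 8, 1, 2, 1, 2, 5, 1, 1, 6, 6, 9, 6, 6] 6 62 ['6', '6'] 90 :=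
    pvA_step1 (by decide) (by decide) (by decide)
  have a67 : pvA_loop ['3', '7'] 36028797018963901 36028797018963878 #[3, 7, 1, 0, 1, 0, 1, 2, 4, 5, 1, 5, 8, 9, 1, 6, 7, 7, 9, 2, 5, 1, 0, 7, 1, 0, 8, 5, 1, 0, 1, 1, 1, 0, 7, 8, 1, 1, 1, 9, 8, 2, 4, 1, 6, 1, 1, 4, 1, 8, 8, 1, 3, 1, 0, 8, 5, 1, 3, 4, 1, 1, 4, 5, 1, 1, 1, 1, 9, 9, 5, 1, 1, 2, 9, 8, 5, 8, 1, 2, 1, 2, 5, 1, 1, 6, 6, 9, 6, 6] 6 62 ['6', '6'] 90 = pvA_loop ['3', '7'] 36028797018963900 36028797018963877 #[3, 7, 1, 0, 1, 0, 1, 2, 4, 5, 1, 5, 8, 9, 1, 6, 7, 7, 9, 2, 5, 1, 0, 7, 1, 0, 8, 5, 1, 0, 1, 1, 1, 0, 7, 8, 1, 1, 1, 9, 8, 2, 4, 1, 6, 1, 1, 4, 1, 8, 8, 1, 3, 1, 0, 8, 5, 1, 3, 4, 1, 1, 4, 5, 1, 1, 1, 1, 9, 9, 5, 1, 1, 2,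 9, 8, 5, 8, 1, 2, 1, 2, 5, 1, 1, 6, 6, 9, 6, 6, 5] 8 67 ['6', '5'] 91 :=
    pvA_step1 (by decide) (by decide) (by decide)
  have a68 : pvA_loop ['3', '7'] 36028797018963900 36028797018963877 #[3, 7, 1, 0, 1, 0, 1, 2, 4, 5, 1, 5, 8, 9, 1, 6, 7, 7, 9, 2, 5, 1, 0, 7, 1, 0, 8, 5, 1, 0, 1, 1, 1, 0, 7, 8, 1, 1, 1, 9, 8, 2, 4, 1, 6, 1, 1, 4, 1, 8, 8, 1, 3, 1, 0, 8, 5, 1, 3, 4, 1, 1, 4, 5, 1, 1, 1, 1, 9, 9, 5, 1, 1, 2, 9, 8, 5, 8, 1, 2, 1, 2, 5, 1, 1, 6, 6, 9, 6, 6, 5] 8 67 ['6', '5'] 91 = pvA_loop ['3', '7'] 36028797018963899 36028797018963876 #[3, 7, 1, 0, 1, 0, 1, 2, 4, 5, 1, 5, 8, 9, 1, 6, 7, 7, 9, 2, 5, 1, 0, 7, 1, 0, 8, 5, 1, 0, 1, 1, 1, 0, 7, 8, 1, 1, 1, 9, 8, 2, 4, 1, 6, 1, 1, 4, 1, 8,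 8, 1, 3, 1, 0, 8, 5, 1, 3, 4, 1, 1, 4, 5, 1, 1, 1, 1, 9, 9, 5, 1, 1, 2, 9, 8, 5, 8, 1, 2, 1, 2, 5, 1, 1, 6, 6, 9, 6, 6, 5, 5] 13 69 ['5', '5'] 92 :=
    pvA_step1 (by decide) (by decide) (by decide)
  have a69 : pvA_loop ['3', '7'] 36028797018963899 36028797018963876 #[3, 7, 1, 0, 1, 0, 1, 2, 4, 5, 1, 5, 8, 9, 1, 6, 7, 7, 9, 2, 5, 1, 0, 7, 1, 0, 8, 5, 1, 0, 1, 1, 1, 0, 7, 8, 1, 1, 1, 9, 8, 2, 4, 1, 6, 1, 1, 4, 1, 8, 8, 1, 3, 1, 0, 8, 5, 1, 3, 4, 1, 1, 4, 5, 1, 1, 1, 1, 9, 9, 5, 1, 1, 2, 9, 8, 5, 8, 1, 2, 1, 2, 5, 1, 1, 6, 6, 9, 6, 6, 5, 5] 13 69 ['5', '5'] 92 = pvA_loop ['3', '7'] 36028797018963898 36028797018963874 #[3, 7, 1, 0, 1, 0, 1, 2, 4, 5, 1, 5, 8, 9, 1, 6, 7, 7, 9, 2, 5, 1, 0, 7,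 1, 0, 8, 5, 1, 0, 1, 1, 1, 0, 7, 8, 1, 1, 1, 9, 8, 2, 4, 1, 6, 1, 1, 4, 1, 8, 8, 1, 3, 1, 0, 8, 5, 1, 3, 4, 1, 1, 4, 5, 1, 1, 1, 1, 9, 9, 5, 1, 1, 2, 9, 8, 5, 8, 1, 2, 1, 2, 5, 1, 1, 6, 6, 9, 6, 6, 5, 5, 1, 8] 23 79 ['1', '8'] 94 :=
    pvA_step1 (by decide) (by decide) (by decide)
  have a70 : pvA_loop ['3', '7'] 36028797018963898 36028797018963874 #[3, 7, 1, 0, 1, 0, 1, 2, 4, 5, 1, 5, 8, 9, 1, 6, 7, 7, 9, 2, 5, 1, 0, 7, 1, 0, 8, 5, 1, 0, 1, 1, 1, 0, 7, 8, 1, 1, 1, 9, 8, 2, 4, 1, 6, 1, 1, 4, 1, 8, 8, 1, 3, 1, 0, 8, 5, 1, 3, 4, 1, 1, 4, 5, 1, 1, 1, 1, 9, 9, 5, 1, 1, 2, 9, 8, 5, 8, 1, 2, 1, 2, 5, 1, 1, 6, 6, 9, 6, 6, 5, 5, 1, 8] 23 79 ['1', '8'] 94 = pvA_loop ['3', '7']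 36028797018963897 36028797018963873 #[3, 7, 1, 0, 1, 0, 1, 2, 4, 5, 1, 5, 8, 9, 1, 6, 7, 7, 9, 2, 5, 1, 0, 7, 1, 0, 8, 5, 1, 0, 1, 1, 1, 0, 7, 8, 1, 1, 1, 9, 8, 2, 4, 1, 6, 1, 1, 4, 1, 8, 8, 1, 3, 1, 0, 8, 5, 1, 3, 4, 1, 1, 4, 5, 1, 1, 1, 1, 9, 9, 5, 1, 1, 2, 9, 8, 5, 8, 1, 2, 1, 2, 5, 1, 1, 6, 6, 9, 6, 6, 5, 5, 1, 8, 9] 31 82 ['8', '9'] 95 :=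
    pvA_step1 (by decide) (by decide) (by decide)
  have a71 : pvA_loop ['3', '7'] 36028797018963897 36028797018963873 #[3, 7, 1, 0, 1, 0, 1, 2, 4, 5, 1, 5, 8, 9, 1, 6, 7, 7, 9, 2, 5, 1, 0, 7, 1, 0, 8, 5, 1, 0, 1, 1, 1, 0, 7, 8, 1, 1, 1, 9, 8, 2, 4, 1, 6, 1, 1, 4, 1, 8, 8, 1, 3, 1, 0, 8, 5, 1, 3, 4, 1, 1, 4, 5, 1, 1, 1, 1, 9, 9, 5, 1, 1, 2, 9, 8, 5, 8, 1, 2, 1, 2, 5, 1, 1, 6, 6, 9, 6, 6, 5, 5, 1, 8, 9] 31 82 ['8', '9'] 95 = pvA_loop ['3', '7'] 36028797018963896 36028797018963872 #[3, 7, 1, 0, 1, 0, 1, 2, 4, 5, 1, 5, 8, 9, 1, 6, 7, 7, 9, 2, 5, 1, 0, 7, 1, 0, 8, 5, 1, 0, 1, 1, 1, 0, 7, 8, 1, 1, 1, 9, 8, 2, 4, 1, 6, 1, 1, 4, 1, 8, 8, 1, 3, 1, 0, 8, 5, 1, 3, 4, 1, 1, 4, 5, 1, 1, 1, 1, 9,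 9, 5, 1, 1, 2, 9, 8, 5, 8, 1, 2, 1, 2, 5, 1, 1, 6, 6, 9, 6, 6, 5, 5, 1, 8, 9, 6] 33 88 ['9', '6'] 96 :=
    pvA_step1 (by decide) (by decide) (by decide)
  have a72 : pvA_loop ['3', '7'] 36028797018963896 36028797018963872 #[3, 7, 1, 0, 1, 0, 1, 2, 4, 5, 1, 5, 8, 9, 1, 6, 7, 7, 9, 2, 5, 1, 0, 7, 1, 0, 8, 5, 1, 0, 1, 1, 1, 0, 7, 8, 1, 1, 1, 9, 8, 2, 4, 1, 6, 1, 1, 4, 1, 8, 8, 1, 3, 1, 0, 8, 5, 1, 3, 4, 1, 1, 4, 5, 1, 1, 1, 1, 9, 9, 5, 1, 1, 2, 9, 8, 5, 8, 1, 2, 1, 2, 5, 1, 1, 6, 6, 9, 6, 6, 5, 5, 1, 8, 9, 6] 33 88 ['9', '6'] 96 = pvA_loop ['3', '7'] 36028797018963895 36028797018963871 #[3, 7, 1, 0, 1, 0, 1, 2, 4, 5, 1, 5, 8, 9, 1, 6, 7, 7, 9, 2, 5, 1, 0, 7, 1, 0, 8, 5, 1, 0, 1, 1, 1, 0, 7,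 8, 1, 1, 1, 9, 8, 2, 4, 1, 6, 1, 1, 4, 1, 8, 8, 1, 3, 1, 0, 8, 5, 1, 3, 4, 1, 1, 4, 5, 1, 1, 1, 1, 9, 9, 5, 1, 1, 2, 9, 8, 5, 8, 1, 2, 1, 2, 5, 1, 1, 6, 6, 9, 6, 6, 5, 5, 1, 8, 9, 6, 6] 34 95 ['6', '6'] 97 :=
    pvA_step1 (by decide) (by decide) (by decide)
  have a73 : pvA_loop ['3', '7'] 36028797018963895 36028797018963871 #[3, 7, 1, 0, 1, 0, 1, 2, 4, 5, 1, 5, 8, 9, 1, 6, 7, 7, 9, 2, 5, 1, 0, 7, 1, 0, 8, 5, 1, 0, 1, 1, 1, 0, 7, 8, 1, 1, 1, 9, 8, 2, 4, 1, 6, 1, 1, 4, 1, 8, 8, 1, 3, 1, 0, 8, 5, 1, 3, 4, 1, 1, 4, 5, 1, 1, 1, 1, 9, 9, 5, 1, 1, 2, 9, 8, 5, 8, 1, 2, 1, 2, 5, 1, 1, 6, 6, 9, 6, 6, 5, 5, 1, 8, 9, 6, 6] 34 95 ['6', '6'] 97 = pvA_loop ['3', '7'] 36028797018963894 36028797018963869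 #[3, 7, 1, 0, 1, 0, 1, 2, 4, 5, 1, 5, 8, 9, 1, 6, 7, 7, 9, 2, 5, 1, 0, 7, 1, 0, 8, 5, 1, 0, 1, 1, 1, 0, 7, 8, 1, 1, 1, 9, 8, 2, 4, 1, 6, 1, 1, 4, 1, 8, 8, 1, 3, 1, 0, 8, 5, 1, 3, 4, 1, 1, 4, 5, 1, 1, 1, 1, 9, 9, 5, 1, 1, 2, 9, 8, 5, 8, 1, 2, 1, 2, 5, 1, 1, 6, 6, 9, 6, 6, 5, 5, 1, 8, 9, 6, 6, 1, 3] 42 3 ['1', '3'] 99 :=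
    pvA_step1 (by decide) (by decide) (by decide)
  have a74 : pvA_loop ['3', '7'] 36028797018963894 36028797018963869 #[3, 7, 1, 0, 1, 0, 1, 2, 4, 5, 1, 5, 8, 9, 1, 6, 7, 7, 9, 2, 5, 1, 0, 7, 1, 0, 8, 5, 1, 0, 1, 1, 1, 0, 7, 8, 1, 1, 1, 9, 8, 2, 4, 1, 6, 1, 1, 4, 1, 8, 8, 1, 3, 1, 0, 8, 5, 1, 3, 4, 1, 1, 4, 5, 1, 1, 1, 1, 9, 9, 5, 1, 1, 2, 9, 8, 5, 8, 1, 2, 1, 2, 5, 1, 1, 6, 6, 9, 6, 6, 5, 5, 1, 8, 9, 6, 6, 1, 3] 42 3 ['1', '3'] 99 = pvA_loop ['3', '7'] 36028797018963893 36028797018963868 #[3, 7, 1, 0, 1, 0, 1, 2, 4, 5, 1, 5, 8, 9, 1, 6, 7, 7, 9, 2, 5, 1, 0, 7, 1, 0, 8, 5, 1, 0, 1, 1, 1, 0, 7, 8, 1, 1, 1, 9, 8, 2, 4, 1, 6, 1, 1, 4, 1, 8, 8, 1, 3, 1, 0, 8, 5, 1, 3, 4, 1, 1, 4, 5, 1,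 1, 1, 1, 9, 9, 5, 1, 1, 2, 9, 8, 5, 8, 1, 2, 1, 2, 5, 1, 1, 6, 6, 9, 6, 6, 5, 5, 1, 8, 9, 6, 6, 1, 3, 4] 47 4 ['3', '4'] 100 :=
    pvA_step1 (by decide) (by decide) (by decide)
  have a75 : pvA_loop ['3', '7'] 36028797018963893 36028797018963868 #[3, 7, 1, 0, 1, 0, 1, 2, 4, 5, 1, 5, 8, 9, 1, 6, 7, 7, 9, 2, 5, 1, 0, 7, 1, 0, 8, 5, 1, 0, 1, 1, 1, 0, 7, 8, 1, 1, 1, 9, 8, 2, 4, 1, 6, 1, 1, 4, 1, 8, 8, 1, 3, 1, 0, 8, 5, 1, 3, 4, 1, 1, 4, 5, 1, 1, 1, 1, 9, 9, 5, 1, 1, 2, 9, 8, 5, 8, 1, 2, 1, 2, 5, 1, 1, 6, 6, 9, 6, 6, 5, 5, 1, 8, 9, 6, 6, 1, 3, 4] 47 4 ['3', '4'] 100 = pvA_loop ['3', '7'] 36028797018963892 36028797018963867 #[3, 7, 1, 0, 1, 0, 1, 2, 4, 5, 1, 5, 8, 9, 1, 6, 7, 7, 9, 2, 5, 1, 0,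 7, 1, 0, 8, 5, 1, 0, 1, 1, 1, 0, 7, 8, 1, 1, 1, 9, 8, 2, 4, 1, 6, 1, 1, 4, 1, 8, 8, 1, 3, 1, 0, 8, 5, 1, 3, 4, 1, 1, 4, 5, 1, 1, 1, 1, 9, 9, 5, 1, 1, 2, 9, 8, 5, 8, 1, 2, 1, 2, 5, 1, 1, 6, 6, 9, 6, 6, 5, 5, 1, 8, 9, 6, 6, 1, 3, 4, 5] 52 6 ['4', '5'] 101 :=
    pvA_step1 (by decide) (by decide) (by decide)
  have a76 : pvA_loop ['3', '7'] 36028797018963892 36028797018963867 #[3, 7, 1, 0, 1, 0, 1, 2, 4, 5, 1, 5, 8, 9, 1, 6, 7, 7, 9, 2, 5, 1, 0, 7, 1, 0, 8, 5, 1, 0, 1, 1, 1, 0, 7, 8, 1, 1, 1, 9, 8, 2, 4, 1, 6, 1, 1, 4, 1, 8, 8, 1, 3, 1, 0, 8, 5, 1, 3, 4, 1, 1, 4, 5, 1, 1, 1, 1, 9, 9, 5, 1, 1, 2, 9, 8, 5, 8, 1, 2, 1, 2, 5, 1, 1, 6, 6, 9, 6, 6, 5, 5, 1, 8, 9, 6,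 6, 1, 3, 4, 5] 52 6 ['4', '5'] 101 = pvA_loop ['3', '7'] 36028797018963891 36028797018963866 #[3, 7, 1, 0, 1, 0, 1, 2, 4, 5, 1, 5, 8, 9, 1, 6, 7, 7, 9, 2, 5, 1, 0, 7, 1, 0, 8, 5, 1, 0, 1, 1, 1, 0, 7, 8, 1, 1, 1, 9, 8, 2, 4, 1, 6, 1, 1, 4, 1, 8, 8, 1, 3, 1, 0, 8, 5, 1, 3, 4, 1, 1, 4, 5, 1, 1, 1, 1, 9, 9, 5, 1, 1, 2, 9, 8, 5, 8, 1, 2, 1, 2, 5, 1, 1, 6, 6, 9, 6, 6, 5, 5, 1, 8, 9, 6, 6, 1, 3, 4, 5, 4] 56 8 ['5', '4'] 102 :=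
    pvA_step1 (by decide) (by decide) (by decide)
  have a77 : pvA_loop ['3', '7'] 36028797018963891 36028797018963866 #[3, 7, 1, 0, 1, 0, 1, 2, 4, 5, 1, 5, 8, 9, 1, 6, 7, 7, 9, 2, 5, 1, 0, 7, 1, 0, 8, 5, 1, 0, 1, 1, 1, 0, 7, 8, 1, 1, 1, 9, 8, 2, 4, 1, 6, 1, 1, 4, 1, 8, 8, 1, 3, 1, 0, 8, 5, 1, 3, 4, 1, 1, 4, 5, 1, 1, 1, 1, 9, 9, 5, 1, 1, 2, 9, 8, 5, 8, 1, 2, 1, 2, 5, 1, 1, 6, 6, 9, 6, 6, 5, 5, 1, 8, 9, 6, 6, 1, 3, 4, 5, 4] 56 8 ['5', '4'] 102 = pvA_loop ['3', '7'] 36028797018963890 36028797018963865 #[3, 7, 1, 0, 1, 0, 1, 2, 4, 5, 1, 5, 8, 9, 1, 6, 7, 7, 9, 2, 5, 1, 0, 7, 1, 0, 8, 5, 1, 0, 1, 1, 1, 0, 7, 8, 1, 1, 1, 9, 8, 2, 4, 1, 6, 1, 1, 4, 1, 8, 8, 1, 3, 1, 0, 8, 5, 1, 3, 4, 1, 1,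 4, 5, 1, 1, 1, 1, 9, 9, 5, 1, 1, 2, 9, 8, 5, 8, 1, 2, 1, 2, 5, 1, 1, 6, 6, 9, 6, 6, 5, 5, 1, 8, 9, 6, 6, 1, 3, 4, 5, 4, 9] 62 13 ['4', '9'] 103 :=
    pvA_step1 (by decide) (by decide) (by decide)
  have a78 : pvA_loop ['3', '7'] 36028797018963890 36028797018963865 #[3, 7, 1, 0, 1, 0, 1, 2, 4, 5, 1, 5, 8, 9, 1, 6, 7, 7, 9, 2, 5, 1, 0, 7, 1, 0, 8, 5, 1, 0, 1, 1, 1, 0, 7, 8, 1, 1, 1, 9, 8, 2, 4, 1, 6, 1, 1, 4, 1, 8, 8, 1, 3, 1, 0, 8, 5, 1, 3, 4, 1, 1, 4, 5, 1, 1, 1, 1, 9, 9, 5, 1, 1, 2, 9, 8, 5, 8, 1, 2, 1, 2, 5, 1, 1, 6, 6, 9, 6, 6, 5, 5, 1, 8, 9, 6, 6, 1, 3, 4, 5, 4, 9] 62 13 ['4', '9'] 103 = pvA_loop ['3', '7'] 36028797018963889 36028797018963863 #[3, 7, 1, 0, 1, 0, 1, 2, 4, 5, 1, 5, 8, 9,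 1, 6, 7, 7, 9, 2, 5, 1, 0, 7, 1, 0, 8, 5, 1, 0, 1, 1, 1, 0, 7, 8, 1, 1, 1, 9, 8, 2, 4, 1, 6, 1, 1, 4, 1, 8, 8, 1, 3, 1, 0, 8, 5, 1, 3, 4, 1, 1, 4, 5, 1, 1, 1, 1, 9, 9, 5, 1, 1, 2, 9, 8, 5, 8, 1, 2, 1, 2, 5, 1, 1, 6, 6, 9, 6, 6, 5, 5, 1, 8, 9, 6, 6, 1, 3, 4, 5, 4, 9, 1, 3] 67 23 ['1', '3'] 105 :=
    pvA_step1 (by decide) (by decide) (by decide)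
  have a79 : pvA_loop ['3', '7'] 36028797018963889 36028797018963863 #[3, 7, 1, 0, 1, 0, 1, 2, 4, 5, 1, 5, 8, 9, 1, 6, 7, 7, 9, 2, 5, 1, 0, 7, 1, 0, 8, 5, 1, 0, 1, 1, 1, 0, 7, 8, 1, 1, 1, 9, 8, 2, 4, 1, 6, 1, 1, 4, 1, 8, 8, 1, 3, 1, 0, 8, 5, 1, 3, 4, 1, 1, 4, 5, 1, 1, 1, 1, 9, 9, 5, 1, 1, 2, 9, 8, 5, 8, 1, 2, 1, 2, 5, 1, 1, 6, 6, 9, 6, 6, 5, 5, 1, 8, 9, 6, 6, 1, 3, 4, 5, 4, 9, 1, 3] 67 23 ['1', '3'] 105 = pvA_loop ['3', '7'] 36028797018963888 36028797018963862 #[3, 7, 1, 0, 1, 0, 1, 2, 4, 5, 1, 5, 8, 9, 1, 6, 7, 7, 9, 2, 5, 1, 0, 7, 1, 0, 8, 5, 1, 0, 1, 1, 1, 0, 7, 8, 1, 1, 1, 9, 8, 2, 4, 1, 6, 1, 1, 4, 1, 8, 8, 1, 3, 1, 0, 8, 5, 1, 3, 4, 1, 1, 4, 5, 1, 1, 1,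 1, 9, 9, 5, 1, 1, 2, 9, 8, 5, 8, 1, 2, 1, 2, 5, 1, 1, 6, 6, 9, 6, 6, 5, 5, 1, 8, 9, 6, 6, 1, 3, 4, 5, 4, 9, 1, 3, 8] 69 31 ['3', '8'] 106 :=
    pvA_step1 (by decide) (by decide) (by decide)
  have a80 : pvA_loop ['3', '7'] 36028797018963888 36028797018963862 #[3, 7, 1, 0, 1, 0, 1, 2, 4, 5, 1, 5, 8, 9, 1, 6, 7, 7, 9, 2, 5, 1, 0, 7, 1, 0, 8, 5, 1, 0, 1, 1, 1, 0, 7, 8, 1, 1, 1, 9, 8, 2, 4, 1, 6, 1, 1, 4, 1, 8, 8, 1, 3, 1, 0, 8, 5, 1, 3, 4, 1, 1, 4, 5, 1, 1, 1, 1, 9, 9, 5, 1, 1, 2, 9, 8, 5, 8, 1, 2, 1, 2, 5, 1, 1, 6, 6, 9, 6, 6, 5, 5, 1, 8, 9, 6, 6, 1, 3, 4, 5, 4, 9, 1, 3, 8] 69 31 ['3', '8'] 106 = pvA_loop ['3', '7'] 36028797018963887 36028797018963860 #[3, 7, 1, 0, 1, 0, 1, 2, 4, 5, 1, 5, 8,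 9, 1, 6, 7, 7, 9, 2, 5, 1, 0, 7, 1, 0, 8, 5, 1, 0, 1, 1, 1, 0, 7, 8, 1, 1, 1, 9, 8, 2, 4, 1, 6, 1, 1, 4, 1, 8, 8, 1, 3, 1, 0, 8, 5, 1, 3, 4, 1, 1, 4, 5, 1, 1, 1, 1, 9, 9, 5, 1, 1, 2, 9, 8, 5, 8, 1, 2, 1, 2, 5, 1, 1, 6, 6, 9, 6, 6, 5, 5, 1, 8, 9, 6, 6, 1, 3, 4, 5, 4, 9, 1, 3, 8, 1, 0] 79 33 ['1', '0'] 108 :=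
    pvA_step1 (by decide) (by decide) (by decide)
  have a81 : pvA_loop ['3', '7'] 36028797018963887 36028797018963860 #[3, 7, 1, 0, 1, 0, 1, 2, 4, 5, 1, 5, 8, 9, 1, 6, 7, 7, 9, 2, 5, 1, 0, 7, 1, 0, 8, 5, 1, 0, 1, 1, 1, 0, 7, 8, 1, 1, 1, 9, 8, 2, 4, 1, 6, 1, 1, 4, 1, 8, 8, 1, 3, 1, 0, 8, 5, 1, 3, 4, 1, 1, 4, 5, 1, 1, 1, 1, 9, 9, 5, 1, 1, 2, 9, 8, 5, 8, 1, 2, 1, 2, 5, 1, 1, 6, 6, 9, 6, 6, 5, 5, 1, 8, 9, 6, 6, 1, 3, 4, 5, 4, 9, 1, 3, 8, 1, 0] 79 33 ['1', '0'] 108 = pvA_loop ['3', '7'] 36028797018963886 36028797018963859 #[3, 7, 1, 0, 1, 0, 1, 2, 4, 5, 1, 5, 8, 9, 1, 6, 7, 7, 9, 2, 5, 1, 0, 7, 1, 0, 8, 5, 1, 0, 1, 1, 1, 0, 7, 8, 1, 1, 1, 9, 8, 2, 4, 1, 6, 1, 1, 4, 1, 8, 8, 1, 3, 1, 0, 8,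 5, 1, 3, 4, 1, 1, 4, 5, 1, 1, 1, 1, 9, 9, 5, 1, 1, 2, 9, 8, 5, 8, 1, 2, 1, 2, 5, 1, 1, 6, 6, 9, 6, 6, 5, 5, 1, 8, 9, 6, 6, 1, 3, 4, 5, 4, 9, 1, 3, 8, 1, 0, 2] 82 34 ['0', '2'] 109 :=
    pvA_step1 (by decide) (by decide) (by decide)
  have a82 : pvA_loop ['3', '7'] 36028797018963886 36028797018963859 #[3, 7, 1, 0, 1, 0, 1, 2, 4, 5, 1, 5, 8, 9, 1, 6, 7, 7, 9, 2, 5, 1, 0, 7, 1, 0, 8, 5, 1, 0, 1, 1, 1, 0, 7, 8, 1, 1, 1, 9, 8, 2, 4, 1, 6, 1, 1, 4, 1, 8, 8, 1, 3, 1, 0, 8, 5, 1, 3, 4, 1, 1, 4, 5, 1, 1, 1, 1, 9, 9, 5, 1, 1, 2, 9, 8, 5, 8, 1, 2, 1, 2, 5, 1, 1, 6, 6, 9, 6, 6, 5, 5, 1, 8, 9, 6, 6, 1, 3, 4, 5, 4, 9, 1, 3, 8, 1, 0, 2] 82 34 ['0', '2'] 109 = pvA_loop ['3', '7'] 36028797018963885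 36028797018963857 #[3, 7, 1, 0, 1, 0, 1, 2, 4, 5, 1, 5, 8, 9, 1, 6, 7, 7, 9, 2, 5, 1, 0, 7, 1, 0, 8, 5, 1, 0, 1, 1, 1, 0, 7, 8, 1, 1, 1, 9, 8, 2, 4, 1, 6, 1, 1, 4, 1, 8, 8, 1, 3, 1, 0, 8, 5, 1, 3, 4, 1, 1, 4, 5, 1, 1, 1, 1, 9, 9, 5, 1, 1, 2, 9, 8, 5, 8, 1, 2, 1, 2, 5, 1, 1, 6, 6, 9, 6, 6, 5, 5, 1, 8, 9, 6, 6, 1, 3, 4, 5, 4, 9, 1, 3, 8, 1, 0, 2, 1, 2] 88 42 ['1', '2'] 111 :=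
    pvA_step1 (by decide) (by decide) (by decide)
  have a83 : pvA_loop ['3', '7'] 36028797018963885 36028797018963857 #[3, 7, 1, 0, 1, 0, 1, 2, 4, 5, 1, 5, 8, 9, 1, 6, 7, 7, 9, 2, 5, 1, 0, 7, 1, 0, 8, 5, 1, 0, 1, 1, 1, 0, 7, 8, 1, 1, 1, 9, 8, 2, 4, 1, 6, 1, 1, 4, 1, 8, 8, 1, 3, 1, 0, 8, 5, 1, 3, 4, 1, 1, 4, 5, 1, 1, 1, 1, 9, 9, 5, 1, 1, 2, 9, 8, 5, 8, 1, 2, 1, 2, 5, 1, 1, 6, 6, 9, 6, 6, 5, 5, 1, 8, 9, 6, 6, 1, 3, 4, 5, 4, 9, 1, 3, 8, 1, 0, 2, 1, 2] 88 42 ['1', '2'] 111 = pvA_loop ['3', '7'] 36028797018963884 36028797018963855 #[3, 7, 1, 0, 1, 0, 1, 2, 4, 5, 1, 5, 8, 9, 1, 6, 7, 7, 9, 2, 5, 1, 0, 7, 1, 0, 8, 5, 1, 0, 1, 1, 1, 0, 7, 8, 1, 1, 1, 9, 8, 2, 4, 1, 6, 1, 1, 4, 1, 8, 8, 1, 3,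 1, 0, 8, 5, 1, 3, 4, 1, 1, 4, 5, 1, 1, 1, 1, 9, 9, 5, 1, 1, 2, 9, 8, 5, 8, 1, 2, 1, 2, 5, 1, 1, 6, 6, 9, 6, 6, 5, 5, 1, 8, 9, 6, 6, 1, 3, 4, 5, 4, 9, 1, 3, 8, 1, 0, 2, 1, 2, 1, 0] 95 47 ['1', '0'] 113 :=
    pvA_step1 (by decide) (by decide) (by decide)
  have a84 : pvA_loop ['3', '7'] 36028797018963884 36028797018963855 #[3, 7, 1, 0, 1, 0, 1, 2, 4, 5, 1, 5, 8, 9, 1, 6, 7, 7, 9, 2, 5, 1, 0, 7, 1, 0, 8, 5, 1, 0, 1, 1, 1, 0, 7, 8, 1, 1, 1, 9, 8, 2, 4, 1, 6, 1, 1, 4, 1, 8, 8, 1, 3, 1, 0, 8, 5, 1, 3, 4, 1, 1, 4, 5, 1, 1, 1, 1, 9, 9, 5, 1, 1, 2, 9, 8, 5, 8, 1, 2, 1, 2, 5, 1, 1, 6, 6, 9, 6, 6, 5, 5, 1, 8, 9, 6, 6, 1, 3, 4, 5, 4, 9, 1, 3, 8, 1, 0, 2, 1, 2, 1, 0] 95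 47 ['1', '0'] 113 = pvA_loop ['3', '7'] 36028797018963883 36028797018963853 #[3, 7, 1, 0, 1, 0, 1, 2, 4, 5, 1, 5, 8, 9, 1, 6, 7, 7, 9, 2, 5, 1, 0, 7, 1, 0, 8, 5, 1, 0, 1, 1, 1, 0, 7, 8, 1, 1, 1, 9, 8, 2, 4, 1, 6, 1, 1, 4, 1, 8, 8, 1, 3, 1, 0, 8, 5, 1, 3, 4, 1, 1, 4, 5, 1, 1, 1, 1, 9, 9, 5, 1, 1, 2, 9, 8, 5, 8, 1, 2, 1, 2, 5, 1, 1, 6, 6, 9, 6, 6, 5, 5, 1, 8, 9, 6, 6, 1, 3, 4, 5, 4, 9, 1, 3, 8, 1, 0, 2, 1, 2, 1, 0, 1, 0] 102 52 ['1', '0'] 115 :=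
    pvA_step1 (by decide) (by decide) (by decide)
  have a85 : pvA_loop ['3', '7'] 36028797018963883 36028797018963853 #[3, 7, 1, 0, 1, 0, 1, 2, 4, 5, 1, 5, 8, 9, 1, 6, 7, 7, 9, 2, 5, 1, 0, 7, 1, 0, 8, 5, 1, 0, 1, 1, 1, 0, 7, 8, 1, 1, 1, 9, 8, 2, 4, 1, 6, 1, 1, 4, 1, 8, 8, 1, 3, 1, 0, 8, 5, 1, 3, 4, 1, 1, 4, 5, 1, 1, 1, 1, 9, 9, 5, 1, 1, 2, 9, 8, 5, 8, 1, 2, 1, 2, 5, 1, 1, 6, 6, 9, 6, 6, 5, 5, 1, 8, 9, 6, 6, 1, 3, 4, 5, 4, 9, 1, 3, 8, 1, 0, 2, 1, 2, 1, 0, 1, 0] 102 52 ['1', '0'] 115 = pvA_loop ['3', '7'] 36028797018963882 36028797018963851 #[3, 7, 1, 0, 1, 0, 1, 2, 4, 5, 1, 5, 8, 9, 1, 6, 7, 7, 9, 2, 5, 1, 0, 7, 1, 0, 8, 5, 1, 0, 1, 1, 1, 0, 7, 8, 1, 1, 1, 9, 8, 2, 4, 1, 6, 1, 1, 4, 1,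 8, 8, 1, 3, 1, 0, 8, 5, 1, 3, 4, 1, 1, 4, 5, 1, 1, 1, 1, 9, 9, 5, 1, 1, 2, 9, 8, 5, 8, 1, 2, 1, 2, 5, 1, 1, 6, 6, 9, 6, 6, 5, 5, 1, 8, 9, 6, 6, 1, 3, 4, 5, 4, 9, 1, 3, 8, 1, 0, 2, 1, 2, 1, 0, 1, 0, 1, 2] 112 56 ['1', '2'] 117 :=
    pvA_step1 (by decide) (by decide) (by decide)
  have a86 : pvA_loop ['3', '7'] 36028797018963882 36028797018963851 #[3, 7, 1, 0, 1, 0, 1, 2, 4, 5, 1, 5, 8, 9, 1, 6, 7, 7, 9, 2, 5, 1, 0, 7, 1, 0, 8, 5, 1, 0, 1, 1, 1, 0, 7, 8, 1, 1, 1, 9, 8, 2, 4, 1, 6, 1, 1, 4, 1, 8, 8, 1, 3, 1, 0, 8, 5, 1, 3, 4, 1, 1, 4, 5, 1, 1, 1, 1, 9, 9, 5, 1, 1, 2, 9, 8, 5, 8, 1, 2, 1, 2, 5, 1, 1, 6, 6, 9, 6, 6, 5, 5, 1, 8, 9, 6, 6, 1, 3, 4, 5, 4, 9, 1, 3, 8,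 1, 0, 2, 1, 2, 1, 0, 1, 0, 1, 2] 112 56 ['1', '2'] 117 = pvA_loop ['3', '7'] 36028797018963881 36028797018963850 #[3, 7, 1, 0, 1, 0, 1, 2, 4, 5, 1, 5, 8, 9, 1, 6, 7, 7, 9, 2, 5, 1, 0, 7, 1, 0, 8, 5, 1, 0, 1, 1, 1, 0, 7, 8, 1, 1, 1, 9, 8, 2, 4, 1, 6, 1, 1, 4, 1, 8, 8, 1, 3, 1, 0, 8, 5, 1, 3, 4, 1, 1, 4, 5, 1, 1, 1, 1, 9, 9, 5, 1, 1, 2, 9, 8, 5, 8, 1, 2, 1, 2, 5, 1, 1, 6, 6, 9, 6, 6, 5, 5, 1, 8, 9, 6, 6, 1, 3, 4, 5, 4, 9, 1, 3, 8, 1, 0, 2, 1, 2, 1, 0, 1, 0, 1, 2, 5] 113 62 ['2', '5'] 118 :=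
    pvA_step1 (by decide) (by decide) (by decide)
  have a87 : pvA_loop ['3', '7'] 36028797018963881 36028797018963850 #[3, 7, 1, 0, 1, 0, 1, 2, 4, 5, 1, 5, 8, 9, 1, 6, 7, 7, 9, 2, 5, 1, 0, 7, 1, 0, 8, 5, 1, 0, 1, 1, 1, 0, 7, 8, 1, 1, 1, 9, 8, 2, 4, 1, 6, 1, 1, 4, 1, 8, 8, 1, 3, 1, 0, 8, 5, 1, 3, 4, 1, 1, 4, 5, 1, 1, 1, 1, 9, 9, 5, 1, 1, 2, 9, 8, 5, 8, 1, 2, 1, 2, 5, 1, 1, 6, 6, 9, 6, 6, 5, 5, 1, 8, 9, 6, 6, 1, 3, 4, 5, 4, 9, 1, 3, 8, 1, 0, 2, 1, 2, 1, 0, 1, 0, 1, 2, 5] 113 62 ['2', '5'] 118 = pvA_loop ['3', '7'] 36028797018963880 36028797018963849 #[3, 7, 1, 0, 1, 0, 1, 2, 4, 5, 1, 5, 8, 9, 1, 6, 7, 7, 9, 2, 5, 1, 0, 7, 1, 0, 8, 5, 1, 0, 1, 1, 1, 0, 7, 8, 1, 1, 1, 9, 8, 2, 4, 1, 6, 1,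 1, 4, 1, 8, 8, 1, 3, 1, 0, 8, 5, 1, 3, 4, 1, 1, 4, 5, 1, 1, 1, 1, 9, 9, 5, 1, 1, 2, 9, 8, 5, 8, 1, 2, 1, 2, 5, 1, 1, 6, 6, 9, 6, 6, 5, 5, 1, 8, 9, 6, 6, 1, 3, 4, 5, 4, 9, 1, 3, 8, 1, 0, 2, 1, 2, 1, 0, 1, 0, 1, 2, 5, 5] 115 67 ['5', '5'] 119 :=
    pvA_step1 (by decide) (by decide) (by decide)
  have a88 : pvA_loop ['3', '7'] 36028797018963880 36028797018963849 #[3, 7, 1, 0, 1, 0, 1, 2, 4, 5, 1, 5, 8, 9, 1, 6, 7, 7, 9, 2, 5, 1, 0, 7, 1, 0, 8, 5, 1, 0, 1, 1, 1, 0, 7, 8, 1, 1, 1, 9, 8, 2, 4, 1, 6, 1, 1, 4, 1, 8, 8, 1, 3, 1, 0, 8, 5, 1, 3, 4, 1, 1, 4, 5, 1, 1, 1, 1, 9, 9, 5, 1, 1, 2, 9, 8, 5, 8, 1, 2, 1, 2, 5, 1, 1, 6, 6, 9, 6, 6, 5, 5, 1, 8, 9, 6, 6, 1, 3, 4, 5,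 4, 9, 1, 3, 8, 1, 0, 2, 1, 2, 1, 0, 1, 0, 1, 2, 5, 5] 115 67 ['5', '5'] 119 = pvA_loop ['3', '7'] 36028797018963879 36028797018963848 #[3, 7, 1, 0, 1, 0, 1, 2, 4, 5, 1, 5, 8, 9, 1, 6, 7, 7, 9, 2, 5, 1, 0, 7, 1, 0, 8, 5, 1, 0, 1, 1, 1, 0, 7, 8, 1, 1, 1, 9, 8, 2, 4, 1, 6, 1, 1, 4, 1, 8, 8, 1, 3, 1, 0, 8, 5, 1, 3, 4, 1, 1, 4, 5, 1, 1, 1, 1, 9, 9, 5, 1, 1, 2, 9, 8, 5, 8, 1, 2, 1, 2, 5, 1, 1, 6, 6, 9, 6, 6, 5, 5, 1, 8, 9, 6, 6, 1, 3, 4, 5, 4, 9, 1, 3, 8, 1, 0, 2, 1, 2, 1, 0, 1, 0, 1, 2, 5, 5, 2] 117 69 ['5', '2'] 120 :=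
    pvA_step1 (by decide) (by decide) (by decide)
  have a89 : pvA_loop ['3', '7'] 36028797018963879 36028797018963848 #[3, 7, 1, 0, 1, 0, 1, 2, 4, 5, 1, 5, 8, 9, 1, 6, 7, 7, 9, 2, 5, 1, 0, 7, 1, 0, 8, 5, 1, 0, 1, 1, 1, 0, 7, 8, 1, 1, 1, 9, 8, 2, 4, 1, 6, 1, 1, 4, 1, 8, 8, 1, 3, 1, 0, 8, 5, 1, 3, 4, 1, 1, 4, 5, 1, 1, 1, 1, 9, 9, 5, 1, 1, 2, 9, 8, 5, 8, 1, 2, 1, 2, 5, 1, 1, 6, 6, 9, 6, 6, 5, 5, 1, 8, 9, 6, 6, 1, 3, 4, 5, 4, 9, 1, 3, 8, 1, 0, 2, 1, 2, 1, 0, 1, 0, 1, 2, 5, 5, 2] 117 69 ['5', '2'] 120 = pvA_loop ['3', '7'] 36028797018963878 36028797018963846 #[3, 7, 1, 0, 1, 0, 1, 2, 4, 5, 1, 5, 8, 9, 1, 6, 7, 7, 9, 2, 5, 1, 0, 7, 1, 0, 8, 5, 1, 0, 1, 1, 1, 0, 7, 8, 1, 1, 1, 9, 8, 2, 4, 1,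 6, 1, 1, 4, 1, 8, 8, 1, 3, 1, 0, 8, 5, 1, 3, 4, 1, 1, 4, 5, 1, 1, 1, 1, 9, 9, 5, 1, 1, 2, 9, 8, 5, 8, 1, 2, 1, 2, 5, 1, 1, 6, 6, 9, 6, 6, 5, 5, 1, 8, 9, 6, 6, 1, 3, 4, 5, 4, 9, 1, 3, 8, 1, 0, 2, 1, 2, 1, 0, 1, 0, 1, 2, 5, 5, 2, 1, 4] 1 79 ['1', '4'] 122 :=
    pvA_step1 (by decide) (by decide) (by decide)
  have a90 : pvA_loop ['3', '7'] 36028797018963878 36028797018963846 #[3, 7, 1, 0, 1, 0, 1, 2, 4, 5, 1, 5, 8, 9, 1, 6, 7, 7, 9, 2, 5, 1, 0, 7, 1, 0, 8, 5, 1, 0, 1, 1, 1, 0, 7, 8, 1, 1, 1, 9, 8, 2, 4, 1, 6, 1, 1, 4, 1, 8, 8, 1, 3, 1, 0, 8, 5, 1, 3, 4, 1, 1, 4, 5, 1, 1, 1, 1, 9, 9, 5, 1, 1, 2, 9, 8, 5, 8, 1, 2, 1, 2, 5, 1, 1, 6, 6, 9, 6, 6, 5, 5, 1, 8, 9, 6,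 6, 1, 3, 4, 5, 4, 9, 1, 3, 8, 1, 0, 2, 1, 2, 1, 0, 1, 0, 1, 2, 5, 5, 2, 1, 4] 1 79 ['1', '4'] 122 = pvA_loop ['3', '7'] 36028797018963877 36028797018963845 #[3, 7, 1, 0, 1, 0, 1, 2, 4, 5, 1, 5, 8, 9, 1, 6, 7, 7, 9, 2, 5, 1, 0, 7, 1, 0, 8, 5, 1, 0, 1, 1, 1, 0, 7, 8, 1, 1, 1, 9, 8, 2, 4, 1, 6, 1, 1, 4, 1, 8, 8, 1, 3, 1, 0, 8, 5, 1, 3, 4, 1, 1, 4, 5, 1, 1, 1, 1, 9, 9, 5, 1, 1, 2, 9, 8, 5, 8, 1, 2, 1, 2, 5, 1, 1, 6, 6, 9, 6, 6, 5, 5, 1, 8, 9, 6, 6, 1, 3, 4, 5, 4, 9, 1, 3, 8, 1, 0, 2, 1, 2, 1, 0, 1, 0, 1, 2, 5, 5, 2, 1, 4, 9] 9 82 ['4', '9'] 123 :=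
    pvA_step1 (by decide) (by decide) (by decide)
  have a91 : pvA_loop ['3', '7'] 36028797018963877 36028797018963845 #[3, 7, 1, 0, 1, 0, 1, 2, 4, 5, 1, 5, 8, 9, 1, 6, 7, 7, 9, 2, 5, 1, 0, 7, 1, 0, 8, 5, 1, 0, 1, 1, 1, 0, 7, 8, 1, 1, 1, 9, 8, 2, 4, 1, 6, 1, 1, 4, 1, 8, 8, 1, 3, 1, 0, 8, 5, 1, 3, 4, 1, 1, 4, 5, 1, 1, 1, 1, 9, 9, 5, 1, 1, 2, 9, 8, 5, 8, 1, 2, 1, 2, 5, 1, 1, 6, 6, 9, 6, 6, 5, 5, 1, 8, 9, 6, 6, 1, 3, 4, 5, 4, 9, 1, 3, 8, 1, 0, 2, 1, 2, 1, 0, 1, 0, 1, 2, 5, 5, 2, 1, 4, 9] 9 82 ['4', '9'] 123 = pvA_loop ['3', '7'] 36028797018963876 36028797018963843 #[3, 7, 1, 0, 1, 0, 1, 2, 4, 5, 1, 5, 8, 9, 1, 6, 7, 7, 9, 2, 5, 1, 0, 7, 1, 0, 8, 5, 1, 0, 1, 1, 1, 0, 7, 8, 1, 1, 1, 9, 8,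 2, 4, 1, 6, 1, 1, 4, 1, 8, 8, 1, 3, 1, 0, 8, 5, 1, 3, 4, 1, 1, 4, 5, 1, 1, 1, 1, 9, 9, 5, 1, 1, 2, 9, 8, 5, 8, 1, 2, 1, 2, 5, 1, 1, 6, 6, 9, 6, 6, 5, 5, 1, 8, 9, 6, 6, 1, 3, 4, 5, 4, 9, 1, 3, 8, 1, 0, 2, 1, 2, 1, 0, 1, 0, 1, 2, 5, 5, 2, 1, 4, 9, 1, 0] 15 88 ['1', '0'] 125 :=
    pvA_step1 (by decide) (by decide) (by decide)
  have a92 : pvA_loop ['3', '7'] 36028797018963876 36028797018963843 #[3, 7, 1, 0, 1, 0, 1, 2, 4, 5, 1, 5, 8, 9, 1, 6, 7, 7, 9, 2, 5, 1, 0, 7, 1, 0, 8, 5, 1, 0, 1, 1, 1, 0, 7, 8, 1, 1, 1, 9, 8, 2, 4, 1, 6, 1, 1, 4, 1, 8, 8, 1, 3, 1, 0, 8, 5, 1, 3, 4, 1, 1, 4, 5, 1, 1, 1, 1, 9, 9, 5, 1, 1, 2, 9, 8, 5, 8, 1, 2, 1, 2, 5, 1, 1, 6, 6, 9, 6, 6,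 5, 5, 1, 8, 9, 6, 6, 1, 3, 4, 5, 4, 9, 1, 3, 8, 1, 0, 2, 1, 2, 1, 0, 1, 0, 1, 2, 5, 5, 2, 1, 4, 9, 1, 0] 15 88 ['1', '0'] 125 = pvA_loop ['3', '7'] 36028797018963875 36028797018963841 #[3, 7, 1, 0, 1, 0, 1, 2, 4, 5, 1, 5, 8, 9, 1, 6, 7, 7, 9, 2, 5, 1, 0, 7, 1, 0, 8, 5, 1, 0, 1, 1, 1, 0, 7, 8, 1, 1, 1, 9, 8, 2, 4, 1, 6, 1, 1, 4, 1, 8, 8, 1, 3, 1, 0, 8, 5, 1, 3, 4, 1, 1, 4, 5, 1, 1, 1, 1, 9, 9, 5, 1, 1, 2, 9, 8, 5, 8, 1, 2, 1, 2, 5, 1, 1, 6, 6, 9, 6, 6, 5, 5, 1, 8, 9, 6, 6, 1, 3, 4, 5, 4, 9, 1, 3, 8, 1, 0, 2, 1, 2, 1, 0, 1, 0, 1, 2, 5, 5, 2, 1, 4, 9, 1, 0, 1, 2] 22 95 ['1', '2'] 127 :=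
    pvA_step1 (by decide) (by decide) (by decide)
  have a93 : pvA_loop ['3', '7'] 36028797018963875 36028797018963841 #[3, 7, 1, 0, 1, 0, 1, 2, 4, 5, 1, 5, 8, 9, 1, 6, 7, 7, 9, 2, 5, 1, 0, 7, 1, 0, 8, 5, 1, 0, 1, 1, 1, 0, 7, 8, 1, 1, 1, 9, 8, 2, 4, 1, 6, 1, 1, 4, 1, 8, 8, 1, 3, 1, 0, 8, 5, 1, 3, 4, 1, 1, 4, 5, 1, 1, 1, 1, 9, 9, 5, 1, 1, 2, 9, 8, 5, 8, 1, 2, 1, 2, 5, 1, 1, 6, 6, 9, 6, 6, 5, 5, 1, 8, 9, 6, 6, 1, 3, 4, 5, 4, 9, 1, 3, 8, 1, 0, 2, 1, 2, 1, 0, 1, 0, 1, 2, 5, 5, 2, 1, 4, 9, 1, 0, 1, 2] 22 95 ['1', '2'] 127 = pvA_loop ['3', '7'] 36028797018963874 36028797018963840 #[3, 7, 1, 0, 1, 0, 1, 2, 4, 5, 1, 5, 8, 9, 1, 6, 7, 7, 9, 2, 5, 1, 0, 7, 1, 0, 8, 5, 1, 0, 1, 1, 1, 0, 7, 8, 1,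 1, 1, 9, 8, 2, 4, 1, 6, 1, 1, 4, 1, 8, 8, 1, 3, 1, 0, 8, 5, 1, 3, 4, 1, 1, 4, 5, 1, 1, 1, 1, 9, 9, 5, 1, 1, 2, 9, 8, 5, 8, 1, 2, 1, 2, 5, 1, 1, 6, 6, 9, 6, 6, 5, 5, 1, 8, 9, 6, 6, 1, 3, 4, 5, 4, 9, 1, 3, 8, 1, 0, 2, 1, 2, 1, 0, 1, 0, 1, 2, 5, 5, 2, 1, 4, 9, 1, 0, 1, 2, 6] 23 102 ['2', '6'] 128 :=
    pvA_step1 (by decide) (by decide) (by decide)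
  have a94 : pvA_loop ['3', '7'] 36028797018963874 36028797018963840 #[3, 7, 1, 0, 1, 0, 1, 2, 4, 5, 1, 5, 8, 9, 1, 6, 7, 7, 9, 2, 5, 1, 0, 7, 1, 0, 8, 5, 1, 0, 1, 1, 1, 0, 7, 8, 1, 1, 1, 9, 8, 2, 4, 1, 6, 1, 1, 4, 1, 8, 8, 1, 3, 1, 0, 8, 5, 1, 3, 4, 1, 1, 4, 5, 1, 1, 1, 1, 9, 9, 5, 1, 1, 2, 9, 8, 5, 8, 1, 2, 1, 2, 5, 1, 1, 6, 6, 9, 6, 6, 5, 5, 1, 8, 9, 6, 6, 1, 3, 4, 5, 4, 9, 1, 3, 8, 1, 0, 2, 1, 2, 1, 0, 1, 0, 1, 2, 5, 5, 2, 1, 4, 9, 1, 0, 1, 2, 6] 23 102 ['2', '6'] 128 = pvA_loop ['3', '7'] 36028797018963873 36028797018963838 #[3, 7, 1, 0, 1, 0, 1, 2, 4, 5, 1, 5, 8, 9, 1, 6, 7, 7, 9, 2, 5, 1, 0, 7, 1, 0, 8, 5, 1, 0, 1, 1, 1, 0, 7, 8, 1, 1, 1, 9, 8, 2, 4, 1,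 6, 1, 1, 4, 1, 8, 8, 1, 3, 1, 0, 8, 5, 1, 3, 4, 1, 1, 4, 5, 1, 1, 1, 1, 9, 9, 5, 1, 1, 2, 9, 8, 5, 8, 1, 2, 1, 2, 5, 1, 1, 6, 6, 9, 6, 6, 5, 5, 1, 8, 9, 6, 6, 1, 3, 4, 5, 4, 9, 1, 3, 8, 1, 0, 2, 1, 2, 1, 0, 1, 0, 1, 2, 5, 5, 2, 1, 4, 9, 1, 0, 1, 2, 6, 1, 6] 31 112 ['1', '6'] 130 :=
    pvA_step1 (by decide) (by decide) (by decide)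
  have a95 : pvA_loop ['3', '7'] 36028797018963873 36028797018963838 #[3, 7, 1, 0, 1, 0, 1, 2, 4, 5, 1, 5, 8, 9, 1, 6, 7, 7, 9, 2, 5, 1, 0, 7, 1, 0, 8, 5, 1, 0, 1, 1, 1, 0, 7, 8, 1, 1, 1, 9, 8, 2, 4, 1, 6, 1, 1, 4, 1, 8, 8, 1, 3, 1, 0, 8, 5, 1, 3, 4, 1, 1, 4, 5, 1, 1, 1, 1, 9, 9, 5, 1, 1, 2, 9, 8, 5, 8, 1, 2, 1, 2, 5, 1, 1, 6, 6, 9, 6, 6, 5, 5, 1, 8, 9, 6, 6, 1, 3, 4, 5, 4, 9, 1, 3, 8, 1, 0, 2, 1, 2, 1, 0, 1, 0, 1, 2, 5, 5, 2, 1, 4, 9, 1, 0, 1, 2, 6, 1, 6] 31 112 ['1', '6'] 130 = pvA_loop ['3', '7'] 36028797018963872 36028797018963837 #[3, 7, 1, 0, 1, 0, 1, 2, 4, 5, 1, 5, 8, 9, 1, 6, 7, 7, 9, 2, 5, 1, 0, 7, 1, 0, 8, 5, 1, 0, 1, 1, 1, 0, 7, 8, 1, 1, 1, 9, 8, 2,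 4, 1, 6, 1, 1, 4, 1, 8, 8, 1, 3, 1, 0, 8, 5, 1, 3, 4, 1, 1, 4, 5, 1, 1, 1, 1, 9, 9, 5, 1, 1, 2, 9, 8, 5, 8, 1, 2, 1, 2, 5, 1, 1, 6, 6, 9, 6, 6, 5, 5, 1, 8, 9, 6, 6, 1, 3, 4, 5, 4, 9, 1, 3, 8, 1, 0, 2, 1, 2, 1, 0, 1, 0, 1, 2, 5, 5, 2, 1, 4, 9, 1, 0, 1, 2, 6, 1, 6, 1] 33 113 ['6', '1'] 131 :=
    pvA_step1 (by decide) (by decide) (by decide)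
  have a96 : pvA_loop ['3', '7'] 36028797018963872 36028797018963837 #[3, 7, 1, 0, 1, 0, 1, 2, 4, 5, 1, 5, 8, 9, 1, 6, 7, 7, 9, 2, 5, 1, 0, 7, 1, 0, 8, 5, 1, 0, 1, 1, 1, 0, 7, 8, 1, 1, 1, 9, 8, 2, 4, 1, 6, 1, 1, 4, 1, 8, 8, 1, 3, 1, 0, 8, 5, 1, 3, 4, 1, 1, 4, 5, 1, 1, 1, 1, 9, 9, 5, 1, 1, 2, 9, 8, 5, 8, 1, 2, 1, 2, 5, 1, 1, 6, 6, 9, 6, 6, 5, 5, 1, 8, 9, 6, 6, 1, 3, 4, 5, 4, 9, 1, 3, 8, 1, 0, 2, 1, 2, 1, 0, 1, 0, 1, 2, 5, 5, 2, 1, 4, 9, 1, 0, 1, 2, 6, 1, 6, 1] 33 113 ['6', '1'] 131 = pvA_loop ['3', '7'] 36028797018963871 36028797018963836 #[3, 7, 1, 0, 1, 0, 1, 2, 4, 5, 1, 5, 8, 9, 1, 6, 7, 7, 9, 2, 5, 1, 0, 7, 1, 0, 8, 5, 1, 0, 1, 1, 1, 0, 7, 8, 1, 1, 1, 9, 8,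 2, 4, 1, 6, 1, 1, 4, 1, 8, 8, 1, 3, 1, 0, 8, 5, 1, 3, 4, 1, 1, 4, 5, 1, 1, 1, 1, 9, 9, 5, 1, 1, 2, 9, 8, 5, 8, 1, 2, 1, 2, 5, 1, 1, 6, 6, 9, 6, 6, 5, 5, 1, 8, 9, 6, 6, 1, 3, 4, 5, 4, 9, 1, 3, 8, 1, 0, 2, 1, 2, 1, 0, 1, 0, 1, 2, 5, 5, 2, 1, 4, 9, 1, 0, 1, 2, 6, 1, 6, 1, 1] 34 115 ['1', '1'] 132 :=
    pvA_step1 (by decide) (by decide) (by decide)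
  have a97 : pvA_loop ['3', '7'] 36028797018963871 36028797018963836 #[3, 7, 1, 0, 1, 0, 1, 2, 4, 5, 1, 5, 8, 9, 1, 6, 7, 7, 9, 2, 5, 1, 0, 7, 1, 0, 8, 5, 1, 0, 1, 1, 1, 0, 7, 8, 1, 1, 1, 9, 8, 2, 4, 1, 6, 1, 1, 4, 1, 8, 8, 1, 3, 1, 0, 8, 5, 1, 3, 4, 1, 1, 4, 5, 1, 1, 1, 1, 9, 9, 5, 1, 1, 2, 9, 8, 5, 8, 1, 2, 1, 2, 5, 1, 1, 6, 6, 9, 6, 6, 5, 5, 1, 8, 9, 6, 6, 1, 3, 4, 5, 4, 9, 1, 3, 8, 1, 0, 2, 1, 2, 1, 0, 1, 0, 1, 2, 5, 5, 2, 1, 4, 9, 1, 0, 1, 2, 6, 1, 6, 1, 1] 34 115 ['1', '1'] 132 = pvA_loop ['3', '7'] 36028797018963870 36028797018963835 #[3, 7, 1, 0, 1, 0, 1, 2, 4, 5, 1, 5, 8, 9, 1, 6, 7, 7, 9, 2, 5, 1, 0, 7, 1, 0, 8, 5, 1, 0, 1, 1, 1, 0, 7, 8, 1, 1, 1, 9,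 8, 2, 4, 1, 6, 1, 1, 4, 1, 8, 8, 1, 3, 1, 0, 8, 5, 1, 3, 4, 1, 1, 4, 5, 1, 1, 1, 1, 9, 9, 5, 1, 1, 2, 9, 8, 5, 8, 1, 2, 1, 2, 5, 1, 1, 6, 6, 9, 6, 6, 5, 5, 1, 8, 9, 6, 6, 1, 3, 4, 5, 4, 9, 1, 3, 8, 1, 0, 2, 1, 2, 1, 0, 1, 0, 1, 2, 5, 5, 2, 1, 4, 9, 1, 0, 1, 2, 6, 1, 6, 1, 1, 8] 42 117 ['1', '8'] 133 :=
    pvA_step1 (by decide) (by decide) (by decide)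
  have a98 : pvA_loop ['3', '7'] 36028797018963870 36028797018963835 #[3, 7, 1, 0, 1, 0, 1, 2, 4, 5, 1, 5, 8, 9, 1, 6, 7, 7, 9, 2, 5, 1, 0, 7, 1, 0, 8, 5, 1, 0, 1, 1, 1, 0, 7, 8, 1, 1, 1, 9, 8, 2, 4, 1, 6, 1, 1, 4, 1, 8, 8, 1, 3, 1, 0, 8, 5, 1, 3, 4, 1, 1, 4, 5, 1, 1, 1, 1, 9, 9, 5, 1, 1, 2, 9, 8, 5, 8, 1, 2, 1, 2, 5, 1, 1, 6, 6, 9, 6, 6, 5, 5, 1, 8, 9, 6, 6, 1, 3, 4, 5, 4, 9, 1, 3, 8, 1, 0, 2, 1, 2, 1, 0, 1, 0, 1, 2, 5, 5, 2, 1, 4, 9, 1, 0, 1, 2, 6, 1, 6, 1, 1, 8] 42 117 ['1', '8'] 133 = pvA_loop ['3', '7'] 36028797018963869 36028797018963834 #[3, 7, 1, 0, 1, 0, 1, 2, 4, 5, 1, 5, 8, 9, 1, 6, 7, 7, 9, 2, 5, 1, 0, 7, 1, 0, 8, 5, 1, 0, 1, 1, 1, 0, 7, 8, 1, 1, 1,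 9, 8, 2, 4, 1, 6, 1, 1, 4, 1, 8, 8, 1, 3, 1, 0, 8, 5, 1, 3, 4, 1, 1, 4, 5, 1, 1, 1, 1, 9, 9, 5, 1, 1, 2, 9, 8, 5, 8, 1, 2, 1, 2, 5, 1, 1, 6, 6, 9, 6, 6, 5, 5, 1, 8, 9, 6, 6, 1, 3, 4, 5, 4, 9, 1, 3, 8, 1, 0, 2, 1, 2, 1, 0, 1, 0, 1, 2, 5, 5, 2, 1, 4, 9, 1, 0, 1, 2, 6, 1, 6, 1, 1, 8, 9] 47 123 ['8', '9'] 134 :=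
    pvA_step1 (by decide) (by decide) (by decide)
  have a99 : pvA_loop ['3', '7'] 36028797018963869 36028797018963834 #[3, 7, 1, 0, 1, 0, 1, 2, 4, 5, 1, 5, 8, 9, 1, 6, 7, 7, 9, 2, 5, 1, 0, 7, 1, 0, 8, 5, 1, 0, 1, 1, 1, 0, 7, 8, 1, 1, 1, 9, 8, 2, 4, 1, 6, 1, 1, 4, 1, 8, 8, 1, 3, 1, 0, 8, 5, 1, 3, 4, 1, 1, 4, 5, 1, 1, 1, 1, 9, 9, 5, 1, 1, 2, 9, 8, 5, 8, 1, 2, 1, 2, 5, 1, 1, 6, 6, 9, 6, 6, 5, 5, 1, 8, 9, 6, 6, 1, 3, 4, 5, 4, 9, 1, 3, 8, 1, 0, 2, 1, 2, 1, 0, 1, 0, 1, 2, 5, 5, 2, 1, 4, 9, 1, 0, 1, 2, 6, 1, 6, 1, 1, 8, 9] 47 123 ['8', '9'] 134 = pvA_loop ['3', '7'] 36028797018963868 36028797018963833 #[3, 7, 1, 0, 1, 0, 1, 2, 4, 5, 1, 5, 8, 9, 1, 6, 7, 7, 9, 2, 5, 1, 0, 7, 1, 0, 8, 5, 1, 0,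 1, 1, 1, 0, 7, 8, 1, 1, 1, 9, 8, 2, 4, 1, 6, 1, 1, 4, 1, 8, 8, 1, 3, 1, 0, 8, 5, 1, 3, 4, 1, 1, 4, 5, 1, 1, 1, 1, 9, 9, 5, 1, 1, 2, 9, 8, 5, 8, 1, 2, 1, 2, 5, 1, 1, 6, 6, 9, 6, 6, 5, 5, 1, 8, 9, 6, 6, 1, 3, 4, 5, 4, 9, 1, 3, 8, 1, 0, 2, 1, 2, 1, 0, 1, 0, 1, 2, 5, 5, 2, 1, 4, 9, 1, 0, 1, 2, 6, 1, 6, 1, 1, 8, 9, 5] 52 125 ['9', '5'] 135 :=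
    pvA_step1 (by decide) (by decide) (by decide)
  have a100 : pvA_loop ['3', '7'] 36028797018963868 36028797018963833 #[3, 7, 1, 0, 1, 0, 1, 2, 4, 5, 1, 5, 8, 9, 1, 6, 7, 7, 9, 2, 5, 1, 0, 7, 1, 0, 8, 5, 1, 0, 1, 1, 1, 0, 7, 8, 1, 1, 1, 9, 8, 2, 4, 1, 6, 1, 1, 4, 1, 8, 8, 1, 3, 1, 0, 8, 5, 1, 3, 4, 1, 1, 4, 5, 1, 1, 1, 1, 9, 9, 5, 1, 1, 2, 9, 8, 5, 8, 1, 2, 1, 2, 5, 1, 1, 6, 6, 9, 6, 6, 5, 5, 1, 8, 9, 6, 6, 1, 3, 4, 5, 4, 9, 1, 3, 8, 1, 0, 2, 1, 2, 1, 0, 1, 0, 1, 2, 5, 5, 2, 1, 4, 9, 1, 0, 1, 2, 6, 1, 6, 1, 1, 8, 9, 5] 52 125 ['9', '5'] 135 = pvA_loop ['3', '7'] 36028797018963867 36028797018963832 #[3, 7, 1, 0, 1, 0, 1, 2, 4, 5, 1, 5, 8, 9, 1, 6, 7, 7, 9, 2, 5, 1, 0, 7, 1, 0, 8, 5, 1,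 0, 1, 1, 1, 0, 7, 8, 1, 1, 1, 9, 8, 2, 4, 1, 6, 1, 1, 4, 1, 8, 8, 1, 3, 1, 0, 8, 5, 1, 3, 4, 1, 1, 4, 5, 1, 1, 1, 1, 9, 9, 5, 1, 1, 2, 9, 8, 5, 8, 1, 2, 1, 2, 5, 1, 1, 6, 6, 9, 6, 6, 5, 5, 1, 8, 9, 6, 6, 1, 3, 4, 5, 4, 9, 1, 3, 8, 1, 0, 2, 1, 2, 1, 0, 1, 0, 1, 2, 5, 5, 2, 1, 4, 9, 1, 0, 1, 2, 6, 1, 6, 1, 1, 8, 9, 5, 4] 56 127 ['5', '4'] 136 :=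
    pvA_step1 (by decide) (by decide) (by decide)
  have a101 : pvA_loop ['3', '7'] 36028797018963867 36028797018963832 #[3, 7, 1, 0, 1, 0, 1, 2, 4, 5, 1, 5, 8, 9, 1, 6, 7, 7, 9, 2, 5, 1, 0, 7, 1, 0, 8, 5, 1, 0, 1, 1, 1, 0, 7, 8, 1, 1, 1, 9, 8, 2, 4, 1, 6, 1, 1, 4, 1, 8, 8, 1, 3, 1, 0, 8, 5, 1, 3, 4, 1, 1, 4, 5, 1, 1, 1, 1, 9, 9, 5, 1, 1, 2, 9, 8, 5, 8, 1, 2, 1, 2, 5, 1, 1, 6, 6, 9, 6, 6, 5, 5, 1, 8, 9, 6, 6, 1, 3, 4, 5, 4, 9, 1, 3, 8, 1, 0, 2, 1, 2, 1, 0, 1, 0, 1, 2, 5, 5, 2, 1, 4, 9, 1, 0, 1, 2, 6, 1, 6, 1, 1, 8, 9, 5, 4] 56 127 ['5', '4'] 136 = pvA_loop ['3', '7'] 36028797018963866 36028797018963830 #[3, 7, 1, 0, 1, 0, 1, 2, 4, 5, 1, 5, 8, 9, 1, 6, 7, 7, 9, 2, 5, 1, 0, 7, 1, 0, 8, 5,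 1, 0, 1, 1, 1, 0, 7, 8, 1, 1, 1, 9, 8, 2, 4, 1, 6, 1, 1, 4, 1, 8, 8, 1, 3, 1, 0, 8, 5, 1, 3, 4, 1, 1, 4, 5, 1, 1, 1, 1, 9, 9, 5, 1, 1, 2, 9, 8, 5, 8, 1, 2, 1, 2, 5, 1, 1, 6, 6, 9, 6, 6, 5, 5, 1, 8, 9, 6, 6, 1, 3, 4, 5, 4, 9, 1, 3, 8, 1, 0, 2, 1, 2, 1, 0, 1, 0, 1, 2, 5, 5, 2, 1, 4, 9, 1, 0, 1, 2, 6, 1, 6, 1, 1, 8, 9, 5, 4, 1, 1] 62 134 ['1', '1'] 138 :=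
    pvA_step1 (by decide) (by decide) (by decide)
  have a102 : pvA_loop ['3', '7'] 36028797018963866 36028797018963830 #[3, 7, 1, 0, 1, 0, 1, 2, 4, 5, 1, 5, 8, 9, 1, 6, 7, 7, 9, 2, 5, 1, 0, 7, 1, 0, 8, 5, 1, 0, 1, 1, 1, 0, 7, 8, 1, 1, 1, 9, 8, 2, 4, 1, 6, 1, 1, 4, 1, 8, 8, 1, 3, 1, 0, 8, 5, 1, 3, 4, 1, 1, 4, 5, 1, 1, 1, 1, 9, 9, 5, 1, 1, 2, 9, 8, 5, 8, 1, 2, 1, 2, 5, 1, 1, 6, 6, 9, 6, 6, 5, 5, 1, 8, 9, 6, 6, 1, 3, 4, 5, 4, 9, 1, 3, 8, 1, 0, 2, 1, 2, 1, 0, 1, 0, 1, 2, 5, 5, 2, 1, 4, 9, 1, 0, 1, 2, 6, 1, 6, 1, 1, 8, 9, 5, 4, 1, 1] 62 134 ['1', '1'] 138 = pvA_loop ['3', '7'] 36028797018963865 36028797018963829 #[3, 7, 1, 0, 1, 0, 1, 2, 4, 5, 1, 5, 8, 9, 1, 6, 7, 7, 9, 2, 5, 1, 0, 7, 1, 0,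 8, 5, 1, 0, 1, 1, 1, 0, 7, 8, 1, 1, 1, 9, 8, 2, 4, 1, 6, 1, 1, 4, 1, 8, 8, 1, 3, 1, 0, 8, 5, 1, 3, 4, 1, 1, 4, 5, 1, 1, 1, 1, 9, 9, 5, 1, 1, 2, 9, 8, 5, 8, 1, 2, 1, 2, 5, 1, 1, 6, 6, 9, 6, 6, 5, 5, 1, 8, 9, 6, 6, 1, 3, 4, 5, 4, 9, 1, 3, 8, 1, 0, 2, 1, 2, 1, 0, 1, 0, 1, 2, 5, 5, 2, 1, 4, 9, 1, 0, 1, 2, 6, 1, 6, 1, 1, 8, 9, 5, 4, 1, 1, 9] 67 1 ['1', '9'] 139 :=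
    pvA_step1 (by decide) (by decide) (by decide)
  have a103 : pvA_loop ['3', '7'] 36028797018963865 36028797018963829 #[3, 7, 1, 0, 1, 0, 1, 2, 4, 5, 1, 5, 8, 9, 1, 6, 7, 7, 9, 2, 5, 1, 0, 7, 1, 0, 8, 5, 1, 0, 1, 1, 1, 0, 7, 8, 1, 1, 1, 9, 8, 2, 4, 1, 6, 1, 1, 4, 1, 8, 8, 1, 3, 1, 0, 8, 5, 1, 3, 4, 1, 1, 4, 5, 1, 1, 1, 1, 9, 9, 5, 1, 1, 2, 9, 8, 5, 8, 1, 2, 1, 2, 5, 1, 1, 6, 6, 9, 6, 6, 5, 5, 1, 8, 9, 6, 6, 1, 3, 4, 5, 4, 9, 1, 3, 8, 1, 0, 2, 1, 2, 1, 0, 1, 0, 1, 2, 5, 5, 2, 1, 4, 9, 1, 0, 1, 2, 6, 1, 6, 1, 1, 8, 9, 5, 4, 1, 1, 9] 67 1 ['1', '9'] 139 = pvA_loop ['3', '7'] 36028797018963864 36028797018963828 #[3, 7, 1, 0, 1, 0, 1, 2, 4, 5, 1, 5, 8, 9, 1, 6, 7, 7, 9, 2, 5, 1, 0, 7, 1,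 0, 8, 5, 1, 0, 1, 1, 1, 0, 7, 8, 1, 1, 1, 9, 8, 2, 4, 1, 6, 1, 1, 4, 1, 8, 8, 1, 3, 1, 0, 8, 5, 1, 3, 4, 1, 1, 4, 5, 1, 1, 1, 1, 9, 9, 5, 1, 1, 2, 9, 8, 5, 8, 1, 2, 1, 2, 5, 1, 1, 6, 6, 9, 6, 6, 5, 5, 1, 8, 9, 6, 6, 1, 3, 4, 5, 4, 9, 1, 3, 8, 1, 0, 2, 1, 2, 1, 0, 1, 0, 1, 2, 5, 5, 2, 1, 4, 9, 1, 0, 1, 2, 6, 1, 6, 1, 1, 8, 9, 5, 4, 1, 1, 9, 8] 69 9 ['9', '8'] 140 :=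
    pvA_step1 (by decide) (by decide) (by decide)
  have a104 : pvA_loop ['3', '7'] 36028797018963864 36028797018963828 #[3, 7, 1, 0, 1, 0, 1, 2, 4, 5, 1, 5, 8, 9, 1, 6, 7, 7, 9, 2, 5, 1, 0, 7, 1, 0, 8, 5, 1, 0, 1, 1, 1, 0, 7, 8, 1, 1, 1, 9, 8, 2, 4, 1, 6, 1, 1, 4, 1, 8, 8, 1, 3, 1, 0, 8, 5, 1, 3, 4, 1, 1, 4, 5, 1, 1, 1, 1, 9, 9, 5, 1, 1, 2, 9, 8, 5, 8, 1, 2, 1, 2, 5, 1, 1, 6, 6, 9, 6, 6, 5, 5, 1, 8, 9, 6, 6, 1, 3, 4, 5, 4, 9, 1, 3, 8, 1, 0, 2, 1, 2, 1, 0, 1, 0, 1, 2, 5, 5, 2, 1, 4, 9, 1, 0, 1, 2, 6, 1, 6, 1, 1, 8, 9, 5, 4, 1, 1, 9, 8] 69 9 ['9', '8'] 140 = pvA_loop ['3', '7'] 36028797018963863 36028797018963826 #[3, 7, 1, 0, 1, 0, 1, 2, 4, 5, 1, 5, 8, 9, 1, 6, 7, 7, 9, 2, 5, 1, 0, 7,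 1, 0, 8, 5, 1, 0, 1, 1, 1, 0, 7, 8, 1, 1, 1, 9, 8, 2, 4, 1, 6, 1, 1, 4, 1, 8, 8, 1, 3, 1, 0, 8, 5, 1, 3, 4, 1, 1, 4, 5, 1, 1, 1, 1, 9, 9, 5, 1, 1, 2, 9, 8, 5, 8, 1, 2, 1, 2, 5, 1, 1, 6, 6, 9, 6, 6, 5, 5, 1, 8, 9, 6, 6, 1, 3, 4, 5, 4, 9, 1, 3, 8, 1, 0, 2, 1, 2, 1, 0, 1, 0, 1, 2, 5, 5, 2, 1, 4, 9, 1, 0, 1, 2, 6, 1, 6, 1, 1, 8, 9, 5, 4, 1, 1, 9, 8, 1, 4] 79 15 ['1', '4'] 142 :=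
    pvA_step1 (by decide) (by decide) (by decide)
  have a105 : pvA_loop ['3', '7'] 36028797018963863 36028797018963826 #[3, 7, 1, 0, 1, 0, 1, 2, 4, 5, 1, 5, 8, 9, 1, 6, 7, 7, 9, 2, 5, 1, 0, 7, 1, 0, 8, 5, 1, 0, 1, 1, 1, 0, 7, 8, 1, 1, 1, 9, 8, 2, 4, 1, 6, 1, 1, 4, 1, 8, 8, 1, 3, 1, 0, 8, 5, 1, 3, 4, 1, 1, 4, 5, 1, 1, 1, 1, 9, 9, 5, 1, 1, 2, 9, 8, 5, 8, 1, 2, 1, 2, 5, 1, 1, 6, 6, 9, 6, 6, 5, 5, 1, 8, 9, 6, 6, 1, 3, 4, 5, 4, 9, 1, 3, 8, 1, 0, 2, 1, 2, 1, 0, 1, 0, 1, 2, 5, 5, 2, 1, 4, 9, 1, 0, 1, 2, 6, 1, 6, 1, 1, 8, 9, 5, 4, 1, 1, 9, 8, 1, 4] 79 15 ['1', '4'] 142 = pvA_loop ['3', '7'] 36028797018963862 36028797018963825 #[3, 7, 1, 0, 1, 0, 1, 2, 4, 5, 1, 5, 8, 9, 1, 6, 7, 7, 9, 2, 5, 1,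 0, 7, 1, 0, 8, 5, 1, 0, 1, 1, 1, 0, 7, 8, 1, 1, 1, 9, 8, 2, 4, 1, 6, 1, 1, 4, 1, 8, 8, 1, 3, 1, 0, 8, 5, 1, 3, 4, 1, 1, 4, 5, 1, 1, 1, 1, 9, 9, 5, 1, 1, 2, 9, 8, 5, 8, 1, 2, 1, 2, 5, 1, 1, 6, 6, 9, 6, 6, 5, 5, 1, 8, 9, 6, 6, 1, 3, 4, 5, 4, 9, 1, 3, 8, 1, 0, 2, 1, 2, 1, 0, 1, 0, 1, 2, 5, 5, 2, 1, 4, 9, 1, 0, 1, 2, 6, 1, 6, 1, 1, 8, 9, 5, 4, 1, 1, 9, 8, 1, 4, 8] 82 22 ['4', '8'] 143 :=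
    pvA_step1 (by decide) (by decide) (by decide)
  have a106 : pvA_loop ['3', '7'] 36028797018963862 36028797018963825 #[3, 7, 1, 0, 1, 0, 1, 2, 4, 5, 1, 5, 8, 9, 1, 6, 7, 7, 9, 2, 5, 1, 0, 7, 1, 0, 8, 5, 1, 0, 1, 1, 1, 0, 7, 8, 1, 1, 1, 9, 8, 2, 4, 1, 6, 1, 1, 4, 1, 8, 8, 1, 3, 1, 0, 8, 5, 1, 3, 4, 1, 1, 4, 5, 1, 1, 1, 1, 9, 9, 5, 1, 1, 2, 9, 8, 5, 8, 1, 2, 1, 2, 5, 1, 1, 6, 6, 9, 6, 6, 5, 5, 1, 8, 9, 6, 6, 1, 3, 4, 5, 4, 9, 1, 3, 8, 1, 0, 2, 1, 2, 1, 0, 1, 0, 1, 2, 5, 5, 2, 1, 4, 9, 1, 0, 1, 2, 6, 1, 6, 1, 1, 8, 9, 5, 4, 1, 1, 9, 8, 1, 4, 8] 82 22 ['4', '8'] 143 = pvA_loop ['3', '7'] 36028797018963861 36028797018963824 #[3, 7, 1, 0, 1, 0, 1, 2, 4, 5, 1, 5, 8, 9, 1, 6, 7, 7, 9, 2, 5,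 1, 0, 7, 1, 0, 8, 5, 1, 0, 1, 1, 1, 0, 7, 8, 1, 1, 1, 9, 8, 2, 4, 1, 6, 1, 1, 4, 1, 8, 8, 1, 3, 1, 0, 8, 5, 1, 3, 4, 1, 1, 4, 5, 1, 1, 1, 1, 9, 9, 5, 1, 1, 2, 9, 8, 5, 8, 1, 2, 1, 2, 5, 1, 1, 6, 6, 9, 6, 6, 5, 5, 1, 8, 9, 6, 6, 1, 3, 4, 5, 4, 9, 1, 3, 8, 1, 0, 2, 1, 2, 1, 0, 1, 0, 1, 2, 5, 5, 2, 1, 4, 9, 1, 0, 1, 2, 6, 1, 6, 1, 1, 8, 9, 5, 4, 1, 1, 9, 8, 1, 4, 8, 5] 88 23 ['8', '5'] 144 :=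
    pvA_step1 (by decide) (by decide) (by decide)
  have a107 : pvA_loop ['3', '7'] 36028797018963861 36028797018963824 #[3, 7, 1, 0, 1, 0, 1, 2, 4, 5, 1, 5, 8, 9, 1, 6, 7, 7, 9, 2, 5, 1, 0, 7, 1, 0, 8, 5, 1, 0, 1, 1, 1, 0, 7, 8, 1, 1, 1, 9, 8, 2, 4, 1, 6, 1, 1, 4, 1, 8, 8, 1, 3, 1, 0, 8, 5, 1, 3, 4, 1, 1, 4, 5, 1, 1, 1, 1, 9, 9, 5, 1, 1, 2, 9, 8, 5, 8, 1, 2, 1, 2, 5, 1, 1, 6, 6, 9, 6, 6, 5, 5, 1, 8, 9, 6, 6, 1, 3, 4, 5, 4, 9, 1, 3, 8, 1, 0, 2, 1, 2, 1, 0, 1, 0, 1, 2, 5, 5, 2, 1, 4, 9, 1, 0, 1, 2, 6, 1, 6, 1, 1, 8, 9, 5, 4, 1, 1, 9, 8, 1, 4, 8, 5] 88 23 ['8', '5'] 144 = pvA_loop ['3', '7'] 36028797018963860 36028797018963822 #[3, 7, 1, 0, 1, 0, 1, 2, 4, 5, 1, 5, 8, 9, 1, 6, 7, 7, 9, 2,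 5, 1, 0, 7, 1, 0, 8, 5, 1, 0, 1, 1, 1, 0, 7, 8, 1, 1, 1, 9, 8, 2, 4, 1, 6, 1, 1, 4, 1, 8, 8, 1, 3, 1, 0, 8, 5, 1, 3, 4, 1, 1, 4, 5, 1, 1, 1, 1, 9, 9, 5, 1, 1, 2, 9, 8, 5, 8, 1, 2, 1, 2, 5, 1, 1, 6, 6, 9, 6, 6, 5, 5, 1, 8, 9, 6, 6, 1, 3, 4, 5, 4, 9, 1, 3, 8, 1, 0, 2, 1, 2, 1, 0, 1, 0, 1, 2, 5, 5, 2, 1, 4, 9, 1, 0, 1, 2, 6, 1, 6, 1, 1, 8, 9, 5, 4, 1, 1, 9, 8, 1, 4, 8, 5, 1, 3] 95 31 ['1', '3'] 146 :=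
    pvA_step1 (by decide) (by decide) (by decide)
  have a108 : pvA_loop ['3', '7'] 36028797018963860 36028797018963822 #[3, 7, 1, 0, 1, 0, 1, 2, 4, 5, 1, 5, 8, 9, 1, 6, 7, 7, 9, 2, 5, 1, 0, 7, 1, 0, 8, 5, 1, 0, 1, 1, 1, 0, 7, 8, 1, 1, 1, 9, 8, 2, 4, 1, 6, 1, 1, 4, 1, 8, 8, 1, 3, 1, 0, 8, 5, 1, 3, 4, 1, 1, 4, 5, 1, 1, 1, 1, 9, 9, 5, 1, 1, 2, 9, 8, 5, 8, 1, 2, 1, 2, 5, 1, 1, 6, 6, 9, 6, 6, 5, 5, 1, 8, 9, 6, 6, 1, 3, 4, 5, 4, 9, 1, 3, 8, 1, 0, 2, 1, 2, 1, 0, 1, 0, 1, 2, 5, 5, 2, 1, 4, 9, 1, 0, 1, 2, 6, 1, 6, 1, 1, 8, 9, 5, 4, 1, 1, 9, 8, 1, 4, 8, 5, 1, 3] 95 31 ['1', '3'] 146 = 145 :=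
    pvA_last (by decide)
  exact (((((((((((((((((((((((((((((((((((((((((((((((((((((((((((((((((((((((((((((((((((((((((((((((((((((((((((((a_init).trans a0).trans a1).trans a2).trans a3).trans a4).trans a5).trans a6).trans a7).trans a8).trans a9).trans a10).trans a11).trans a12).trans a13).trans a14).trans a15).trans a16).trans a17).trans a18).trans a19).trans a20).trans a21).trans a22).trans a23).trans a24).trans a25).trans a26).trans a27).trans a28).trans a29).trans a30).trans a31).trans a32).trans a33).trans a34).trans a35).trans a36).trans a37).trans a38).trans a39).trans a40).trans a41).trans a42).trans a43).trans a44).trans a45).trans a46).trans a47).trans a48).trans a49).trans a50).trans a51).trans a52).trans a53).trans a54).trans a55).trans a56).trans a57).trans a58).trans a59).trans a60).trans a61).trans a62).trans a63).trans a64).trans a65).trans a66).trans a67).trans a68).trans a69).trans a70).trans a71).trans a72).trans a73).trans a74).trans a75).trans a76).trans a77).trans a78).trans a79).trans a80).trans a81).trans a82).trans a83).trans a84).trans a85).trans a86).trans a87).trans a88).trans a89).trans a90).trans a91).trans a92).trans a93).trans a94).trans a95).trans a96).trans a97).trans a98).trans a99).trans a100).trans a101).trans a102).trans a103).trans a104).trans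 a105).trans a106).trans a107).trans a108
-- a two-digit target found from end position 3 onwards yields a positive answer, never 0
lemma pv_ans_ne (tl : List Int) (hlen : tl.length = 2) :
    ∀ lo, 3 ≤ lo → pvAnsFrom tl lo ≠ 0 := by
  intro lo
  obtain ⟨d, hd⟩ : ∃ d, pvN + 1 - lo = d := ⟨_, rfl⟩
  induction d generalizing lo with
  | zero =>
    intro h3
    rw [pvAnsFrom_stop tl (by omega)]
    norm_num
  | succ d ih =>
    intro h3
    rw [pvAnsFrom_step tl (by omega)]
    cases hm : pvMatchEndB tl lo
    · rw [if_neg (by simp)]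
      exact ih (lo + 1) (by omega) (by omega)
    · rw [if_pos rfl, hlen]
      intro hcon
      omega

-- ===== VERDICT (by name: the statements are the Claim_ definitions above) =====

theorem get_part_two_answer_spec : Claim_unchanged_get_part_two_answer := by
  intro x _ hpre hD
  exact pv_main x hpre (fun h => hD h)

set_option maxRecDepth 10000 in
theorem get_part_two_answer_changed : Claim_changed_get_part_two_answer := by
  unfold Claim_changed_get_part_two_answer
  refine ⟨by decide, by decide, by decide, pv_A_at_37, pv_B_at_37, by decide⟩

theorem get_part_two_answer_tight : Claim_exact_get_part_two_answer := by
  intro x _ hpre hD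
  have hD' : PySem.Int.toChars x = ['3', '7'] := hD
  have htl37 : (PySem.Int.toChars x).map (fun c => ((c.toNat : Int) - 48)) = [3, 7] := by
    rw [hD']
    decide
  rw [pv_A_eq x hpre, pv_B_eq x hpre, htl37]
  have hm2 : pvMatchEndB [3, 7] 2 = true := by
    unfold pvMatchEndB
    apply decide_eq_true
    rw [pv_full_take2]
    rfl
  have hB0 : pvAnsFrom [3, 7] (([3, 7] : List Int).length) = 0 := by
    rw [show (([3, 7] : List Int).length) = 2 from rfl,
      pvAnsFrom_step _ (by unfold pvN; norm_num), if_pos hm2]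
    norm_num
  rw [hB0]
  exact pv_ans_ne [3, 7] rfl 3 (by norm_num)
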